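import Lean.Meta.Tactic.Simp.RegisterCommand
/-
PySem — Python-exact primitives for the program-equivalence environment (pv_equiv).

A Lean port of a Python function should compute what the Python computes on every
admitted input. Ports diverge from their Python almost always at a dozen built-ins
(negative indexing, slicing, // and % with a negative divisor, dict overwrite order,
int() parsing, stable sort, min/max ties, the whitespace/digit/case sets of str), not
in the algorithm. This module implements exactly those built-ins with CPython's
semantics (reference: CPython 3.13), so a port can call them instead of re-inventing
them. Where Python RAISES, the primitive returns `Option` (none = the exception) and a
decidable side condition in `PySem.Raise` names the inputs on which it does not, for
the port's `Pre_`.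

Core Lean plus one Lean-frontend module for the `pysem` simp-set registration (no Mathlib import): it compiles in about a minute wherever the grader runs.
Every definition is computable; the `@[simp]` lemmas and the bridge lemmas reduce the
primitives to the usual List/Int/String functions under the side condition that makes
them agree, so proofs about honest ports stay in familiar territory. String functions
are exact on the environment's stated input domain (printable ASCII); outside it the
Unicode tables are not modelled in this version.

GRADER CODE: kernel-checked, differentially tested against CPython (tests/), trusted.
-/

/-- The `pysem` simp set: every PySem lemma (tagged at the end of PySem.lean — an attribute cannot be used in the module that
registers it), so `simp only [pysem]` / `simp [pysem, …]` tries the whole prelude book without the author knowing each name.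
(This import is the one non-core dependency of this file; it costs ≈50 s of compile per container — a third tiny module would
avoid it and is the planned refinement.) -/
register_simp_attr pysem


namespace PySem

/-! ## Raise — the side conditions under which Python's raising operations return -/
namespace Raise

/-- `xs[i]` does not raise IndexError: `-len ≤ i < len`. -/
def InRange (n : Nat) (i : Int) : Prop := -(n : Int) ≤ i ∧ i < n
instance (n : Nat) (i : Int) : Decidable (InRange n i) := by unfold InRange; exact inferInstance

end Raise

/-! ## Int — floor division and modulo with Python's sign rules, int()/str() -/
namespace Int

/-- Python `a // b` (floor toward −∞). `b = 0` raises ZeroDivisionError in Python; here it is `none`. -/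
def floordiv? (a b : _root_.Int) : Option _root_.Int := if b = 0 then none else some (a.fdiv b)
/-- Python `a // b` for a divisor known to be non-zero (state `b ≠ 0` in Pre_). -/
def floordiv (a b : _root_.Int) : _root_.Int := a.fdiv b
/-- Python `a % b` (result has the sign of the DIVISOR). -/
def mod? (a b : _root_.Int) : Option _root_.Int := if b = 0 then none else some (a.fmod b)
def mod (a b : _root_.Int) : _root_.Int := a.fmod b
/-- Python `divmod(a, b)`. -/
def divmod? (a b : _root_.Int) : Option (_root_.Int × _root_.Int) :=
  if b = 0 then none else some (a.fdiv b, a.fmod b)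
/-- Python `int(a / b)` for integers small enough that the float division is exact (|a|,|b| < 2^53): truncation toward zero. -/
def truncdiv (a b : _root_.Int) : _root_.Int := a.tdiv b

@[simp] theorem floordiv_eq_ediv_of_pos {a b : _root_.Int} (h : 0 < b) : floordiv a b = a / b := by
  unfold floordiv; exact Int.fdiv_eq_ediv_of_nonneg _ (Int.le_of_lt h)
@[simp] theorem mod_eq_emod_of_pos {a b : _root_.Int} (h : 0 < b) : mod a b = a % b := by
  unfold mod; exact Int.fmod_eq_emod_of_nonneg _ (Int.le_of_lt h)
theorem floordiv?_of_ne_zero {a b : _root_.Int} (h : b ≠ 0) : floordiv? a b = some (floordiv a b) := by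
  simp [floordiv?, floordiv, h]
theorem mod?_of_ne_zero {a b : _root_.Int} (h : b ≠ 0) : mod? a b = some (mod a b) := by
  simp [mod?, mod, h]

-- ---- lemma pack 3: // and % at naturals, bounds of %
/-- m // k on naturals is Nat division (also at k = 0: both sides are 0). -/
@[simp] theorem floordiv_natCast (m k : Nat) : floordiv (m : _root_.Int) (k : _root_.Int) = ((m / k : Nat) : _root_.Int) := by
  unfold floordiv; rw [Int.fdiv_eq_ediv_of_nonneg _ (by omega)]; simp
/-- m % k on naturals is Nat modulo. -/
@[simp] theorem mod_natCast (m k : Nat) : mod (m : _root_.Int) (k : _root_.Int) = ((m % k : Nat) : _root_.Int) := by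
  unfold mod; rw [Int.fmod_eq_emod_of_nonneg _ (by omega)]; simp
theorem mod_nonneg (a : _root_.Int) {b : _root_.Int} (h : 0 < b) : 0 ≤ mod a b := by
  rw [mod_eq_emod_of_pos h]; exact Int.emod_nonneg _ (by omega)
theorem mod_lt (a : _root_.Int) {b : _root_.Int} (h : 0 < b) : mod a b < b := by
  rw [mod_eq_emod_of_pos h]; exact Int.emod_lt_of_pos _ h
/-- a == (a // b) * b + a % b — Python's invariant, for EVERY b (also negative; at b = 0 both sides are a here). -/
theorem floordiv_mul_add_mod (a b : _root_.Int) : floordiv a b * b + mod a b = a := by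
  unfold floordiv mod; rw [Int.add_comm]; exact Int.fmod_add_fdiv_mul a b
/-- a % b for a NEGATIVE divisor lies in (b, 0] — the sign-of-the-divisor rule. -/
theorem mod_neg_bounds (a : _root_.Int) {b : _root_.Int} (h : b < 0) : b < mod a b ∧ mod a b ≤ 0 := by
  unfold mod; rw [Int.fmod_eq_emod]
  have hne : b ≠ 0 := by omega
  have h0 := Int.emod_nonneg a hne
  have h1 := Int.emod_lt a hne
  have hb : (b.natAbs : _root_.Int) = -b := Int.ofNat_natAbs_of_nonpos (by omega)
  rw [hb] at h1
  split
  · rename_i hd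
    have hd' : b ∣ a := hd.resolve_left (by omega)
    rw [Int.emod_eq_zero_of_dvd hd']; omega
  · rename_i hd
    have : a % b ≠ 0 := fun he => hd (Or.inr (Int.dvd_of_emod_eq_zero he))
    omega
/-- the midpoint of lo ≤ hi lies between them (binary search). -/
theorem floordiv_two_mid_bounds {lo hi : _root_.Int} (h : lo ≤ hi) : lo ≤ floordiv (lo + hi) 2 ∧ floordiv (lo + hi) 2 ≤ hi := by
  rw [floordiv_eq_ediv_of_pos (by omega)]; omega

/-! ### Lemma pack 4 — % as divisibility, the // bracket (floor and ceiling) -/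
/-- 'a % b == 0' is divisibility — for EVERY b (at b = 0 both sides say a = 0). -/
theorem mod_eq_zero_iff_dvd (a b : _root_.Int) : mod a b = 0 ↔ b ∣ a := by
  unfold mod; rw [Int.fmod_eq_emod]
  split
  · simp [Int.dvd_iff_emod_eq_zero]
  · rename_i h
    have hb : b < 0 := by omega
    have hnd : ¬ b ∣ a := fun hd => h (Or.inr hd)
    have h0 := Int.emod_nonneg a (show b ≠ 0 by omega)
    have h1 := Int.emod_lt a (show b ≠ 0 by omega)
    have hb' : (b.natAbs : _root_.Int) = -b := Int.ofNat_natAbs_of_nonpos (by omega)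
    rw [hb'] at h1
    have : a % b ≠ 0 := fun he => hnd (Int.dvd_of_emod_eq_zero he)
    constructor
    · intro he; omega
    · intro hd; exact absurd hd hnd
/-- the same once 'simp' has already turned mod into core's % (it does whenever 0 < b is at hand): a % b = 0 is divisibility too. -/
theorem emod_eq_zero_iff_dvd (a b : _root_.Int) : a % b = 0 ↔ b ∣ a := ⟨Int.dvd_of_emod_eq_zero, Int.emod_eq_zero_of_dvd⟩
theorem mod?_eq_some_zero_iff_dvd {a b : _root_.Int} (hb : b ≠ 0) : mod? a b = some 0 ↔ b ∣ a := by
  rw [mod?_of_ne_zero hb, Option.some.injEq, mod_eq_zero_iff_dvd]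
/-- characterising a // b for b > 0 by the bracket q*b ≤ a < (q+1)*b (and its two halves). -/
theorem le_floordiv_iff_mul_le {a b q : _root_.Int} (hb : 0 < b) : q ≤ floordiv a b ↔ q * b ≤ a := by
  rw [floordiv_eq_ediv_of_pos hb]; exact Int.le_ediv_iff_mul_le hb
theorem floordiv_lt_iff_lt_mul {a b q : _root_.Int} (hb : 0 < b) : floordiv a b < q ↔ a < q * b := by
  rw [floordiv_eq_ediv_of_pos hb]; exact Int.ediv_lt_iff_lt_mul hb
theorem floordiv_eq_iff_of_pos {a b q : _root_.Int} (hb : 0 < b) : floordiv a b = q ↔ q * b ≤ a ∧ a < (q + 1) * b := by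
  rw [← le_floordiv_iff_mul_le hb, ← floordiv_lt_iff_lt_mul hb]; omega
/-- ceiling division spelled -((-a) // b): the bracket (q-1)*b < a ≤ q*b. -/
theorem neg_floordiv_neg_eq_iff_of_pos {a b q : _root_.Int} (hb : 0 < b) : -(floordiv (-a) b) = q ↔ (q - 1) * b < a ∧ a ≤ q * b := by
  have h := @floordiv_eq_iff_of_pos (-a) b (-q) hb
  rw [Int.neg_mul, show (-q + 1) * b = -((q - 1) * b) by rw [← Int.neg_mul]; congr 1; omega] at h
  omega
/-! ### Lemma pack 6 — sign reflection of // and %, // on non-negatives, parity, pow with a modulus -/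
/-- (-a) // (-b) == a // b (for every b; at b = 0 both sides are 0). -/
@[simp] theorem floordiv_neg_neg (a b : _root_.Int) : floordiv (-a) (-b) = floordiv a b := by
  unfold floordiv; exact Int.neg_fdiv_neg a b
/-- (-a) % (-b) == -(a % b) (the sign-of-the-divisor rule, reflected). -/
@[simp] theorem mod_neg_neg (a b : _root_.Int) : mod (-a) (-b) = -(mod a b) := by
  unfold mod; exact Int.neg_fmod_neg a b
/-- a // b ≥ 0 when a, b ≥ 0. -/
theorem floordiv_nonneg {a b : _root_.Int} (ha : 0 ≤ a) (hb : 0 ≤ b) : 0 ≤ floordiv a b := by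
  unfold floordiv; exact Int.fdiv_nonneg ha hb
/-- a // b for 0 ≤ b (any a) is core's a / b (floor = Euclidean for a non-negative divisor; also at b = 0). Cite by name: not in the simp set. -/
theorem floordiv_of_nonneg {a b : _root_.Int} (hb : 0 ≤ b) : floordiv a b = a / b := by
  unfold floordiv; exact Int.fdiv_eq_ediv_of_nonneg _ hb
/-- a % b for 0 ≤ b is core's a % b. -/
theorem mod_of_nonneg (a : _root_.Int) {b : _root_.Int} (hb : 0 ≤ b) : mod a b = a % b := by
  unfold mod; exact Int.fmod_eq_emod_of_nonneg _ hb
/-- a % 2 is 0 or 1. -/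
theorem mod_two_eq (a : _root_.Int) : mod a 2 = 0 ∨ mod a 2 = 1 := by
  unfold mod; exact Int.fmod_two_eq a
/-- a // b * b == a exactly when b divides a (b ≠ 0 not needed: at b = 0 both say a = 0). -/
theorem floordiv_mul_eq_self_iff_dvd (a b : _root_.Int) : floordiv a b * b = a ↔ b ∣ a := by
  have h := floordiv_mul_add_mod a b
  rw [← mod_eq_zero_iff_dvd]; omega

/-- Python pow(b, e, m) for e ≥ 0 and m ≠ 0: (b ** e) % m, sign of m (state 'm ≠ 0 ∧ 0 ≤ e' in Pre_; a negative e is the modular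
inverse, not modelled). -/
def powMod (b : _root_.Int) (e : Nat) (m : _root_.Int) : _root_.Int := mod (b ^ e) m
theorem powMod_eq (b : _root_.Int) (e : Nat) (m : _root_.Int) : powMod b e m = mod (b ^ e) m := rfl
theorem powMod_eq_emod (b : _root_.Int) (e : Nat) {m : _root_.Int} (hm : 0 < m) : powMod b e m = b ^ e % m := by
  rw [powMod, mod_eq_emod_of_pos hm]
theorem powMod_nonneg (b : _root_.Int) (e : Nat) {m : _root_.Int} (hm : 0 < m) : 0 ≤ powMod b e m := mod_nonneg _ hm
theorem powMod_lt (b : _root_.Int) (e : Nat) {m : _root_.Int} (hm : 0 < m) : powMod b e m < m := mod_lt _ hm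

/-! ### Pack 5 — int.bit_length() / int.bit_count() (Python-exact on negatives: both look at |n|). Structural on a fuel argument, so
'decide' / 'rfl' evaluate them and the halving lemmas below are plain inductions. Lean core's bitwise operators on Int — n <<< k, n >>> k,
and ~~~n / Int.not — already have Python's infinite-two's-complement semantics; use them directly. -/
def bitLengthAux : Nat → Nat → Nat
  | 0, _ => 0
  | f + 1, n => if n = 0 then 0 else bitLengthAux f (n / 2) + 1
def bitCountAux : Nat → Nat → Nat
  | 0, _ => 0
  | f + 1, n => if n = 0 then 0 else n % 2 + bitCountAux f (n / 2)
/-- Python 'n.bit_length()': binary digits of |n| (0 for 0). -/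
def bitLength (n : _root_.Int) : Nat := bitLengthAux (n.natAbs + 1) n.natAbs
/-- Python 'n.bit_count()': ones in the binary expansion of |n|. -/
def bitCount (n : _root_.Int) : Nat := bitCountAux (n.natAbs + 1) n.natAbs

private theorem bitLengthAux_stable : ∀ (f g n : Nat), n < f → n < g → bitLengthAux f n = bitLengthAux g n
  | 0, _, _, hf, _ => absurd hf (Nat.not_lt_zero _)
  | _, 0, _, _, hg => absurd hg (Nat.not_lt_zero _)
  | f + 1, g + 1, n, hf, hg => by
    simp only [bitLengthAux]
    split
    · rfl
    · rw [bitLengthAux_stable f g (n / 2) (by omega) (by omega)]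
private theorem bitCountAux_stable : ∀ (f g n : Nat), n < f → n < g → bitCountAux f n = bitCountAux g n
  | 0, _, _, hf, _ => absurd hf (Nat.not_lt_zero _)
  | _, 0, _, _, hg => absurd hg (Nat.not_lt_zero _)
  | f + 1, g + 1, n, hf, hg => by
    simp only [bitCountAux]
    split
    · rfl
    · rw [bitCountAux_stable f g (n / 2) (by omega) (by omega)]
@[simp] theorem bitLength_zero : bitLength 0 = 0 := rfl
@[simp] theorem bitCount_zero : bitCount 0 = 0 := rfl
@[simp] theorem bitLength_neg (n : _root_.Int) : bitLength (-n) = bitLength n := by simp [bitLength]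
@[simp] theorem bitCount_neg (n : _root_.Int) : bitCount (-n) = bitCount n := by simp [bitCount]
/-- the halving recursion Python code uses ('while n: n >>= 1; c += 1'): for a natural m, bit_length(m) = bit_length(m // 2) + 1 (m > 0). -/
private theorem bitLength_natCast' (m : Nat) : bitLength (m : _root_.Int) = if m = 0 then 0 else bitLength ((m / 2 : Nat) : _root_.Int) + 1 := by
  simp only [bitLength, Int.natAbs_natCast]
  rw [bitLengthAux]
  split
  · rfl
  · rw [bitLengthAux_stable m (m / 2 + 1) (m / 2) (by omega) (by omega)]
private theorem bitCount_natCast' (m : Nat) : bitCount (m : _root_.Int) = if m = 0 then 0 else m % 2 + bitCount ((m / 2 : Nat) : _root_.Int) := by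
  simp only [bitCount, Int.natAbs_natCast]
  rw [bitCountAux]
  split
  · rfl
  · rw [bitCountAux_stable m (m / 2 + 1) (m / 2) (by omega) (by omega)]
@[simp] theorem bitLength_natCast_zero : bitLength ((0 : Nat) : _root_.Int) = 0 := rfl
@[simp] theorem bitCount_natCast_zero : bitCount ((0 : Nat) : _root_.Int) = 0 := rfl
theorem bitLength_natCast {m : Nat} (h : 0 < m) : bitLength (m : _root_.Int) = bitLength ((m / 2 : Nat) : _root_.Int) + 1 := by
  rw [bitLength_natCast', if_neg (by omega)]
theorem bitCount_natCast {m : Nat} (h : 0 < m) : bitCount (m : _root_.Int) = m % 2 + bitCount ((m / 2 : Nat) : _root_.Int) := by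
  rw [bitCount_natCast', if_neg (by omega)]
/-- the same at a non-negative Int with Python's // (floordiv by 2). -/
theorem bitLength_of_pos {n : _root_.Int} (h : 0 < n) : bitLength n = bitLength (floordiv n 2) + 1 := by
  obtain ⟨m, rfl⟩ := Int.eq_ofNat_of_zero_le (Int.le_of_lt h)
  rw [bitLength_natCast (by omega), floordiv_eq_ediv_of_pos (by decide), show (m : _root_.Int) / 2 = ((m / 2 : Nat) : _root_.Int) by omega]
theorem bitCount_of_pos {n : _root_.Int} (h : 0 < n) : bitCount n = (mod n 2).toNat + bitCount (floordiv n 2) := by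
  obtain ⟨m, rfl⟩ := Int.eq_ofNat_of_zero_le (Int.le_of_lt h)
  rw [bitCount_natCast (by omega), floordiv_eq_ediv_of_pos (by decide), mod_eq_emod_of_pos (by decide),
    show (m : _root_.Int) / 2 = ((m / 2 : Nat) : _root_.Int) by omega, show (m : _root_.Int) % 2 = ((m % 2 : Nat) : _root_.Int) by omega, Int.toNat_natCast]
/-- bit_length brackets |n|: 2^(b-1) ≤ |n| < 2^b (n ≠ 0), and bit_length 0 = 0. -/
theorem lt_two_pow_bitLength (n : _root_.Int) : n.natAbs < 2 ^ bitLength n := by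
  suffices H : ∀ (k m : Nat), m < 2 ^ k → m < 2 ^ bitLength (m : _root_.Int) by
    have := H n.natAbs n.natAbs (Nat.lt_two_pow_self)
    simpa [bitLength] using this
  intro k
  induction k with
  | zero => intro m hm; rw [bitLength_natCast']; split <;> simp_all
  | succ k ih =>
    intro m hm
    rw [bitLength_natCast']
    split
    · simp_all
    · have := ih (m / 2) (by omega)
      rw [Nat.pow_succ]; omega
theorem two_pow_bitLength_le (n : _root_.Int) (h : n ≠ 0) : 2 ^ (bitLength n - 1) ≤ n.natAbs := by
  suffices H : ∀ (k m : Nat), m < 2 ^ k → m ≠ 0 → 2 ^ (bitLength (m : _root_.Int) - 1) ≤ m by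
    have := H n.natAbs n.natAbs (Nat.lt_two_pow_self) (by omega)
    simpa [bitLength] using this
  intro k
  induction k with
  | zero => intro m hm h0; omega
  | succ k ih =>
    intro m hm h0
    rw [bitLength_natCast (by omega)]
    by_cases h1 : m / 2 = 0
    · rw [h1]; simp; omega
    · have := ih (m / 2) (by omega) h1
      have hb : bitLength ((m / 2 : Nat) : _root_.Int) ≠ 0 := by rw [bitLength_natCast (by omega)]; omega
      rw [show bitLength ((m / 2 : Nat) : _root_.Int) + 1 - 1 = (bitLength ((m / 2 : Nat) : _root_.Int) - 1) + 1 by omega, Nat.pow_succ]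
      omega
theorem bitCount_le_bitLength (n : _root_.Int) : bitCount n ≤ bitLength n := by
  suffices H : ∀ (k m : Nat), m < 2 ^ k → bitCount (m : _root_.Int) ≤ bitLength (m : _root_.Int) by
    have := H n.natAbs n.natAbs (Nat.lt_two_pow_self); simpa [bitLength, bitCount] using this
  intro k
  induction k with
  | zero => intro m hm; rw [bitLength_natCast', bitCount_natCast']; split <;> simp_all
  | succ k ih => intro m hm; rw [bitLength_natCast', bitCount_natCast']; split; simp; have := ih (m / 2) (by omega); omega
/-! ### Pack 6 — Python's & | ^ on ints (infinite two's complement), exact on negatives, via core Nat's &&& ||| ^^^ (decide-reducible).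
A negative operand a is ~a' with a' = -a-1 ≥ 0; De Morgan then leaves one Nat operation per sign case. -/
/-- Python 'a & b'. -/
def band (a b : _root_.Int) : _root_.Int :=
  if 0 ≤ a then
    if 0 ≤ b then ((a.toNat &&& b.toNat : Nat) : _root_.Int)
    else ((a.toNat - (a.toNat &&& (-b - 1).toNat) : Nat) : _root_.Int)
  else
    if 0 ≤ b then ((b.toNat - (b.toNat &&& (-a - 1).toNat) : Nat) : _root_.Int)
    else -(((-a - 1).toNat ||| (-b - 1).toNat : Nat) : _root_.Int) - 1
/-- Python 'a | b'. -/
def bor (a b : _root_.Int) : _root_.Int :=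
  if 0 ≤ a then
    if 0 ≤ b then ((a.toNat ||| b.toNat : Nat) : _root_.Int)
    else -(((-b - 1).toNat - ((-b - 1).toNat &&& a.toNat) : Nat) : _root_.Int) - 1
  else
    if 0 ≤ b then -(((-a - 1).toNat - ((-a - 1).toNat &&& b.toNat) : Nat) : _root_.Int) - 1
    else -(((-a - 1).toNat &&& (-b - 1).toNat : Nat) : _root_.Int) - 1
/-- Python 'a ^ b'. -/
def bxor (a b : _root_.Int) : _root_.Int :=
  if 0 ≤ a then
    if 0 ≤ b then ((a.toNat ^^^ b.toNat : Nat) : _root_.Int)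
    else -((a.toNat ^^^ (-b - 1).toNat : Nat) : _root_.Int) - 1
  else
    if 0 ≤ b then -(((-a - 1).toNat ^^^ b.toNat : Nat) : _root_.Int) - 1
    else (((-a - 1).toNat ^^^ (-b - 1).toNat : Nat) : _root_.Int)

/-- on naturals these ARE Nat's operators. -/
@[simp] theorem band_natCast (m n : Nat) : band (m : _root_.Int) (n : _root_.Int) = ((m &&& n : Nat) : _root_.Int) := by simp [band]
@[simp] theorem bor_natCast (m n : Nat) : bor (m : _root_.Int) (n : _root_.Int) = ((m ||| n : Nat) : _root_.Int) := by simp [bor]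
@[simp] theorem bxor_natCast (m n : Nat) : bxor (m : _root_.Int) (n : _root_.Int) = ((m ^^^ n : Nat) : _root_.Int) := by simp [bxor]
theorem band_of_nonneg {a b : _root_.Int} (ha : 0 ≤ a) (hb : 0 ≤ b) : band a b = ((a.toNat &&& b.toNat : Nat) : _root_.Int) := by simp [band, ha, hb]
theorem bor_of_nonneg {a b : _root_.Int} (ha : 0 ≤ a) (hb : 0 ≤ b) : bor a b = ((a.toNat ||| b.toNat : Nat) : _root_.Int) := by simp [bor, ha, hb]
theorem bxor_of_nonneg {a b : _root_.Int} (ha : 0 ≤ a) (hb : 0 ≤ b) : bxor a b = ((a.toNat ^^^ b.toNat : Nat) : _root_.Int) := by simp [bxor, ha, hb]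
theorem band_nonneg_of_nonneg_left {a : _root_.Int} (b : _root_.Int) (ha : 0 ≤ a) : 0 ≤ band a b := by
  unfold band; simp only [ha, ↓reduceIte]; split <;> omega
theorem band_comm (a b : _root_.Int) : band a b = band b a := by
  unfold band; split <;> split <;> simp_all [Nat.and_comm, Nat.or_comm] <;> omega
theorem bor_comm (a b : _root_.Int) : bor a b = bor b a := by
  unfold bor; split <;> split <;> simp_all [Nat.and_comm, Nat.or_comm] <;> omega
theorem bxor_comm (a b : _root_.Int) : bxor a b = bxor b a := by
  unfold bxor; split <;> split <;> simp_all [Nat.xor_comm] <;> omega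
@[simp] theorem band_zero (a : _root_.Int) : band a 0 = 0 := by unfold band; split <;> simp
@[simp] theorem bor_zero (a : _root_.Int) : bor a 0 = a := by unfold bor; split <;> simp <;> omega
@[simp] theorem bxor_zero (a : _root_.Int) : bxor a 0 = a := by unfold bxor; split <;> simp <;> omega
@[simp] theorem bxor_self (a : _root_.Int) : bxor a a = 0 := by unfold bxor; split <;> simp
@[simp] theorem band_self (a : _root_.Int) : band a a = a := by unfold band; split <;> simp [Nat.and_self, Nat.or_self] <;> omega
@[simp] theorem band_neg_one (a : _root_.Int) : band a (-1) = a := by unfold band; split <;> simp <;> omega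
/-- a & 1 is a % 2 (Python, every sign). -/
theorem band_one (a : _root_.Int) : band a 1 = mod a 2 := by
  unfold band mod
  have h1 : (0 : _root_.Int) ≤ 1 := by decide
  simp only [h1, ↓reduceIte]
  rw [Int.fmod_eq_emod_of_nonneg _ (by decide)]
  split
  · rename_i ha; rw [show (1 : _root_.Int).toNat = 1 by rfl, Nat.and_one_is_mod]; omega
  · rename_i ha; rw [show (1 : _root_.Int).toNat = 1 by rfl]
    have : (1 &&& (-a - 1).toNat : Nat) = (-a - 1).toNat % 2 := by rw [Nat.and_comm, Nat.and_one_is_mod]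
    rw [this]; omega

/-! Every string-valued primitive below is DEFINED over `List Char` (kernel-transparent: `decide`/`rfl` reduce it and
lemmas unfold it) and the `String` form is a thin wrapper through `String.toList` / `String.ofList` — Lean 4.29's own String
operations (length, append, isEmpty, extract, …) are opaque constants the kernel cannot unfold. -/

/-- The characters Python's `int()` strips around the digits (str.isspace minus U+001C–U+001F), ASCII part. -/
def isIntSpace (c : Char) : Bool :=
  c = ' ' || c = '\t' || c = '\n' || c = '\r' || c = '\x0b' || c = '\x0c'

private def digitsVal? : List Char → Option Nat
  | [] => none
  | cs =>
    -- digits with single underscores BETWEEN digits ('1_000'); no leading/trailing/double underscore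
    let rec go : List Char → Bool → Nat → Option Nat
      | [], afterDigit, acc => if afterDigit then some acc else none
      | c :: rest, afterDigit, acc =>
        if c.isDigit then go rest true (acc * 10 + (c.toNat - '0'.toNat))
        else if c = '_' ∧ afterDigit then
          match rest with
          | d :: _ => if d.isDigit then go rest false acc else none
          | [] => none
        else none
    go cs false 0

/-- Python `int(s)` for base 10 over the characters of s: optional surrounding whitespace, optional sign, ASCII digits with
single underscores between them. `none` = ValueError. (Unicode digits are outside the stated domain.) -/
def ofChars? (s : _root_.List Char) : Option _root_.Int :=
  let cs := (s.dropWhile isIntSpace).reverse.dropWhile isIntSpace |>.reverse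
  match cs with
  | '-' :: ds => (digitsVal? ds).map (fun n => -(n : _root_.Int))
  | '+' :: ds => (digitsVal? ds).map (fun n => (n : _root_.Int))
  | ds => (digitsVal? ds).map (fun n => (n : _root_.Int))

/-- Python `int(s)`. -/
def ofStr? (s : String) : Option _root_.Int := ofChars? s.toList

/-! ### Pack 5 — int(s, base) for base 0 / 2..36 (ASCII). -/
/-- the value of one ASCII digit/letter in bases up to 36 ('7' ↦ 7, 'a'/'A' ↦ 10, …, 'z'/'Z' ↦ 35). -/
def digitVal? (c : Char) : Option Nat :=
  if c.isDigit then some (c.toNat - 48)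
  else if 'a' ≤ c ∧ c ≤ 'z' then some (c.toNat - 87)
  else if 'A' ≤ c ∧ c ≤ 'Z' then some (c.toNat - 55)
  else none
private def digitOk (b : Nat) (c : Char) : Bool := match digitVal? c with | some d => decide (d < b) | none => false
/-- digits in base b with single underscores BETWEEN digits; at least one digit. -/
private def digitsValB? (b : Nat) : _root_.List Char → Option Nat
  | [] => none
  | cs =>
    let rec go : _root_.List Char → Bool → Nat → Option Nat
      | [], afterDigit, acc => if afterDigit then some acc else none
      | c :: rest, afterDigit, acc =>
        if digitOk b c then go rest true (acc * b + (digitVal? c).getD 0)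
        else if c = '_' ∧ afterDigit then
          match rest with
          | d :: _ => if digitOk b d then go rest false acc else none
          | [] => none
        else none
    go cs false 0
/-- Python 'int(s, base)' for base = 0 or 2 ≤ base ≤ 36 over the characters of s: surrounding whitespace, a sign, an optional 0b/0o/0x prefix
when it names the base (base 0 takes the base FROM the prefix, else 10 — and then refuses leading zeros: int('010', 0) raises), single
underscores between digits (and one right after a prefix), digits 0-9 a-z A-Z below the base. none = ValueError (also for a bad base).
(int(s) with no base is ofChars? = ofCharsBase? s 10; Unicode digits are outside the stated domain.) -/
def ofCharsBase? (s : _root_.List Char) (base : _root_.Int) : Option _root_.Int :=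
  if ¬ (base = 0 ∨ (2 ≤ base ∧ base ≤ 36)) then none else
  let cs := (s.dropWhile isIntSpace).reverse.dropWhile isIntSpace |>.reverse
  let (neg, cs) : Bool × _root_.List Char := match cs with
    | '-' :: r => (true, r)
    | '+' :: r => (false, r)
    | r => (false, r)
  let pfx : Option Nat := match cs with
    | '0' :: c :: _ => if c = 'b' ∨ c = 'B' then some 2 else if c = 'o' ∨ c = 'O' then some 8 else if c = 'x' ∨ c = 'X' then some 16 else none
    | _ => none
  let usePfx : Bool := match pfx with | some p => base = 0 ∨ base.toNat = p | none => false
  let b : Nat := if usePfx then pfx.getD 10 else if base = 0 then 10 else base.toNat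
  -- '0b_1' is fine (one underscore right after a prefix) but '0b_' / '0b__1' are not
  let ds := if usePfx then (match cs.drop 2 with | '_' :: d :: r => if digitOk b d then d :: r else '_' :: d :: r | r => r) else cs
  match digitsValB? b ds with
  | none => none
  | some n =>
    if base = 0 ∧ ¬ usePfx ∧ n ≠ 0 ∧ ds.head? = some '0' then none
    else some (if neg then -(n : _root_.Int) else (n : _root_.Int))
/-- Python 'int(s, base)'. -/
def ofStrBase? (s : String) (base : _root_.Int) : Option _root_.Int := ofCharsBase? s.toList base
@[simp] theorem ofStrBase?_ofList (cs : _root_.List Char) (b : _root_.Int) : ofStrBase? (String.ofList cs) b = ofCharsBase? cs b := by simp [ofStrBase?]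


/-- Python `str(n)` as characters: a leading '-' for negatives, then the decimal digits (Nat.toDigits — kernel-transparent). -/
def toChars (n : _root_.Int) : _root_.List Char :=
  if n < 0 then '-' :: Nat.toDigits 10 n.natAbs else Nat.toDigits 10 n.toNat

/-- Python `str(n)` for an int. -/
def toStr (n : _root_.Int) : String := String.ofList (toChars n)

@[simp] theorem toList_toStr (n : _root_.Int) : (toStr n).toList = toChars n := by simp [toStr]

/-- Python `format(n, 'b')` / `f"{n:b}"` as characters: the binary digits of |n| (Nat.toDigits 2 — kernel-transparent; "0" for 0),
with a leading '-' for negatives. NOT `bin(n)` (that one carries the "0b" prefix: `toBinChars0b`). -/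
def toBinChars (n : _root_.Int) : _root_.List Char :=
  if n < 0 then '-' :: Nat.toDigits 2 n.natAbs else Nat.toDigits 2 n.toNat

/-- Python `format(n, 'b')`. -/
def toBin (n : _root_.Int) : String := String.ofList (toBinChars n)

/-- Python `bin(n)` as characters: "0b" + binary digits, "-0b…" for negatives. -/
def toBinChars0b (n : _root_.Int) : _root_.List Char :=
  if n < 0 then '-' :: '0' :: 'b' :: Nat.toDigits 2 n.natAbs else '0' :: 'b' :: Nat.toDigits 2 n.toNat

/-- Python `bin(n)`. -/
def pyBin (n : _root_.Int) : String := String.ofList (toBinChars0b n)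

@[simp] theorem toList_toBin (n : _root_.Int) : (toBin n).toList = toBinChars n := by simp [toBin]
@[simp] theorem toList_pyBin (n : _root_.Int) : (pyBin n).toList = toBinChars0b n := by simp [pyBin]
@[simp] theorem ofStr?_ofList (cs : _root_.List Char) : ofStr? (String.ofList cs) = ofChars? cs := by simp [ofStr?]

end Int

/-! ## List — indexing and slicing with negative indices, stable sorted, min/max ties, pop -/
namespace List

variable {α : Type}

/-- The position a Python index denotes: negative indices count from the end. `none` = IndexError. -/
def pyIdx? (n : Nat) (i : _root_.Int) : Option Nat :=
  if 0 ≤ i then (if i < n then some i.toNat else none)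
  else (if -(n : _root_.Int) ≤ i then some (n - (-i).toNat) else none)

/-- Python `xs[i]`: negative `i` counts from the end; `none` = IndexError. -/
def pyGet? (xs : _root_.List α) (i : _root_.Int) : Option α :=
  (pyIdx? xs.length i).bind fun k => xs[k]?

/-- Python `xs[i]` with a default instead of IndexError — ONLY for ports whose Pre_ states `Raise.InRange xs.length i`. -/
def pyGetD (xs : _root_.List α) (i : _root_.Int) (d : α) : α := (pyGet? xs i).getD d

/-- Python `xs[i] = v` (a new list); `none` = IndexError. -/
def pySet? (xs : _root_.List α) (i : _root_.Int) (v : α) : Option (_root_.List α) :=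
  (pyIdx? xs.length i).map fun k => xs.set k v

@[simp] theorem pyGet?_of_nonneg_of_lt (xs : _root_.List α) {i : _root_.Int} (h0 : 0 ≤ i) (h1 : i < xs.length) :
    pyGet? xs i = xs[i.toNat]? := by
  simp [pyGet?, pyIdx?, h0, h1]
theorem pyGet?_neg (xs : _root_.List α) {i : _root_.Int} (h0 : i < 0) (h1 : -(xs.length : _root_.Int) ≤ i) :
    pyGet? xs i = xs[xs.length - (-i).toNat]? := by
  have : ¬ 0 ≤ i := Int.not_le.mpr h0
  simp [pyGet?, pyIdx?, this, h1]
theorem pyGet?_eq_none_iff (xs : _root_.List α) (i : _root_.Int) :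
    pyGet? xs i = none ↔ ¬ Raise.InRange xs.length i := by
  simp only [pyGet?, pyIdx?, Raise.InRange]
  split <;> split <;> simp <;> omega

/-- CPython `slice.indices`: the concrete (start, stop, step) a slice denotes for a sequence of length n. step ≠ 0. -/
def sliceIndices (n : Nat) (start? stop? : Option _root_.Int) (step : _root_.Int) : _root_.Int × _root_.Int × _root_.Int :=
  let len : _root_.Int := n
  let lower : _root_.Int := if step < 0 then -1 else 0
  let upper : _root_.Int := if step < 0 then len - 1 else len
  let clamp (x? : Option _root_.Int) (dflt : _root_.Int) : _root_.Int :=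
    match x? with
    | none => dflt
    | some x => if x < 0 then max (x + len) lower else min x upper
  let start := clamp start? (if step < 0 then upper else lower)
  let stop := clamp stop? (if step < 0 then lower else upper)
  (start, stop, step)

/-- Python `xs[start:stop:step]` (any of the three may be omitted; negative bounds count from the end and clamp;
a negative step walks backwards). `none` = ValueError (step 0). -/
def slice? (xs : _root_.List α) (start? stop? : Option _root_.Int := none) (step : _root_.Int := 1) : Option (_root_.List α) :=
  if step = 0 then none else
  let (s, e, st) := sliceIndices xs.length start? stop? step
  -- the element positions visited, in order
  let count : Nat :=
    if 0 < st then (if s < e then ((e - s + st - 1) / st).toNat else 0)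
    else (if e < s then ((s - e + (-st) - 1) / (-st)).toNat else 0)
  some ((_root_.List.range count).filterMap fun (k : Nat) => xs[(s + st * (k : _root_.Int)).toNat]?)

/-- The position a step-1 slice BOUND denotes (CPython slice.indices with step 1): negative counts from the end, then clamp to [0, n]. -/
def clampIdx (n : Nat) (i : _root_.Int) : Nat :=
  if i < 0 then (if (n : _root_.Int) + i < 0 then 0 else ((n : _root_.Int) + i).toNat) else min i.toNat n

/-- Python `xs[start:stop]` with step 1 (never raises): drop to the clamped start, take up to the clamped stop. Defined directly
as drop/take so proofs meet ordinary List lemmas at once; `slice?` below is the general stepped form (they agree on step 1 —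
differentially tested). -/
def slice (xs : _root_.List α) (start? stop? : Option _root_.Int := none) : _root_.List α :=
  let a := match start? with | none => 0 | some i => clampIdx xs.length i
  let b := match stop? with | none => xs.length | some i => clampIdx xs.length i
  (xs.drop a).take (b - a)

@[simp] theorem slice_none_none (xs : _root_.List α) : slice xs none none = xs := by simp [slice]
@[simp] theorem clampIdx_of_nonneg_of_le {n : Nat} {i : _root_.Int} (h0 : 0 ≤ i) (h1 : i ≤ n) : clampIdx n i = i.toNat := by
  have : ¬ i < 0 := Int.not_lt.mpr h0
  simp [clampIdx, this]; omega
theorem slice_of_nonneg (xs : _root_.List α) {a b : _root_.Int} (ha : 0 ≤ a) (hb : 0 ≤ b) (han : a ≤ xs.length) (hbn : b ≤ xs.length) :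
    slice xs (some a) (some b) = (xs.drop a.toNat).take (b.toNat - a.toNat) := by
  simp [slice, clampIdx_of_nonneg_of_le ha han, clampIdx_of_nonneg_of_le hb hbn]
@[simp] theorem clampIdx_of_nonneg {n : Nat} {i : _root_.Int} (h0 : 0 ≤ i) : clampIdx n i = min i.toNat n := by
  have : ¬ i < 0 := Int.not_lt.mpr h0
  simp [clampIdx, this]
/-- `xs[:b]` for any b ≥ 0 (b past the end clamps, as take does). -/
theorem slice_to (xs : _root_.List α) {b : _root_.Int} (hb : 0 ≤ b) : slice xs none (some b) = xs.take b.toNat := by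
  simp [slice, clampIdx_of_nonneg hb, _root_.List.take_eq_take_iff]
/-- `xs[a:]` for any a ≥ 0. -/
theorem slice_from (xs : _root_.List α) {a : _root_.Int} (ha : 0 ≤ a) : slice xs (some a) none = xs.drop a.toNat := by
  simp [slice, clampIdx_of_nonneg ha]
  by_cases h : a.toNat ≤ xs.length
  · simp [Nat.min_eq_left h, _root_.List.take_of_length_le]
  · have h' : xs.length ≤ a.toNat := by omega
    simp [Nat.min_eq_right h', _root_.List.drop_of_length_le h']

/-- Python `range(start, stop, step)` as a list (step ≠ 0; `[]` for step 0 here — state `step ≠ 0` in Pre_). -/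
def pyRange (start stop : _root_.Int) (step : _root_.Int := 1) : _root_.List _root_.Int :=
  if step = 0 then [] else
  let count : Nat :=
    if 0 < step then (if start < stop then ((stop - start + step - 1) / step).toNat else 0)
    else (if stop < start then ((start - stop + (-step) - 1) / (-step)).toNat else 0)
  (_root_.List.range count).map fun (k : Nat) => start + step * (k : _root_.Int)

/-- `range(a, b)` (step 1) is the arithmetic progression from a of length (b - a).toNat. -/
theorem pyRange_one (a b : _root_.Int) : pyRange a b 1 = (_root_.List.range (b - a).toNat).map fun (k : Nat) => a + (k : _root_.Int) := by
  unfold pyRange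
  by_cases h : a < b
  · simp [h]
  · have : (b - a).toNat = 0 := by omega
    simp [h, this]
/-- `range(n)` = 0, 1, …, n-1. -/
theorem pyRange_zero (n : _root_.Int) : pyRange 0 n 1 = (_root_.List.range n.toNat).map fun (k : Nat) => (k : _root_.Int) := by
  simp [pyRange_one]
@[simp] theorem length_pyRange_one (a b : _root_.Int) : (pyRange a b 1).length = (b - a).toNat := by simp [pyRange_one]

/-- Python `xs.index(v)`: first position, `none` = ValueError. -/
def index? [BEq α] (xs : _root_.List α) (v : α) : Option Nat := xs.idxOf? v
/-- Python `xs.count(v)`. -/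
def count [BEq α] (xs : _root_.List α) (v : α) : Nat := xs.count v
/-- Python `xs.insert(i, v)`: i clamps like a slice bound (never raises). -/
def insert (xs : _root_.List α) (i : _root_.Int) (v : α) : _root_.List α :=
  let (k, _, _) := sliceIndices xs.length (some i) none 1
  xs.take k.toNat ++ v :: xs.drop k.toNat
/-- Python `xs.pop(i)` (default last): (element, remaining list); `none` = IndexError (incl. empty list). -/
def pop? (xs : _root_.List α) (i : _root_.Int := -1) : Option (α × _root_.List α) :=
  (pyIdx? xs.length i).bind fun k => xs[k]?.map fun x => (x, xs.eraseIdx k)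
/-- Python `xs.remove(v)`: first occurrence removed; `none` = ValueError. -/
def remove? [BEq α] (xs : _root_.List α) (v : α) : Option (_root_.List α) :=
  (xs.idxOf? v).map fun k => xs.eraseIdx k

/-- Stable insertion of x into an already-ordered list: x goes AFTER every element it does not strictly precede. -/
def insertBy (before : α → α → Bool) (x : α) : _root_.List α → _root_.List α
  | [] => [x]
  | y :: ys => if before x y then x :: y :: ys else y :: insertBy before x ys
/-- Python `sorted(xs, key=key, reverse=reverse)`: STABLE; with reverse=True elements with equal keys keep their
original relative order (it is not `reverse ∘ sorted`). The key type needs a decidable `<`. A structural insertion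
sort (kernel-transparent: `decide` evaluates it; core's mergeSort is well-founded and does not reduce in the kernel). -/
def sorted {κ : Type} [LT κ] [DecidableLT κ] (xs : _root_.List α) (key : α → κ) (reverse : Bool := false) : _root_.List α :=
  let before : α → α → Bool := if reverse then (fun a b => key b < key a) else (fun a b => key a < key b)  -- strict: equal keys keep input order
  xs.foldl (fun acc x => insertBy before x acc) []

theorem insertBy_perm (before : α → α → Bool) (x : α) (ys : _root_.List α) : (insertBy before x ys).Perm (x :: ys) := by
  induction ys with
  | nil => simp [insertBy]
  | cons y ys ih =>
    simp only [insertBy]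
    split
    · exact _root_.List.Perm.refl _
    · exact (_root_.List.Perm.cons y ih).trans (_root_.List.Perm.swap x y ys)
theorem foldl_insertBy_perm (before : α → α → Bool) (xs acc : _root_.List α) :
    (xs.foldl (fun acc x => insertBy before x acc) acc).Perm (acc ++ xs) := by
  induction xs generalizing acc with
  | nil => simp
  | cons x xs ih =>
    simp only [_root_.List.foldl_cons]
    refine (ih _).trans ?_
    exact ((insertBy_perm before x acc).append_right xs).trans (by simpa using _root_.List.perm_middle.symm)
/-- `sorted` is a permutation of its input (whatever the key and direction). -/
theorem sorted_perm {κ : Type} [LT κ] [DecidableLT κ] (xs : _root_.List α) (key : α → κ) (rev : Bool) : (sorted xs key rev).Perm xs := by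
  unfold sorted
  generalize (if rev = true then fun a b => decide (key b < key a) else fun a b => decide (key a < key b)) = before
  suffices h : ∀ (acc : _root_.List α), (xs.foldl (fun acc x => insertBy before x acc) acc).Perm (acc ++ xs) by simpa using h []
  induction xs with
  | nil => intro acc; simp
  | cons x xs ih =>
    intro acc
    simp only [_root_.List.foldl_cons]
    refine (ih _).trans ?_
    have hp := (insertBy_perm before x acc).append_right xs
    refine hp.trans ?_
    simpa using _root_.List.perm_middle.symm
/-- Python `sorted(xs, key=lambda x: (k1(x), k2(x)), reverse=…)`: a TWO-LEVEL (tuple) key, compared lexicographically as Python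
compares tuples. Use this for tuple keys — do NOT write `fun x => (k1 x, k2 x)` as a key to `sorted`: with Mathlib imported, `<` on
pairs is the pointwise order, not Python's lexicographic one. Ties on both levels keep input order; reverse as for `sorted`. -/
def sorted2 {κ₁ κ₂ : Type} [LT κ₁] [DecidableLT κ₁] [LT κ₂] [DecidableLT κ₂]
    (xs : _root_.List α) (k1 : α → κ₁) (k2 : α → κ₂) (reverse : Bool := false) : _root_.List α :=
  let lt : α → α → Bool := fun a b => k1 a < k1 b || (!(k1 b < k1 a) && k2 a < k2 b)  -- (k1 a, k2 a) < (k1 b, k2 b) lexicographically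
  let before : α → α → Bool := if reverse then (fun a b => lt b a) else lt
  xs.foldl (fun acc x => insertBy before x acc) []
/-- `min(xs, key=lambda x: (k1(x), k2(x)))` / `max(…)`: first extremal element under the two-level key. -/
def min2? {κ₁ κ₂ : Type} [LT κ₁] [DecidableLT κ₁] [LT κ₂] [DecidableLT κ₂] (xs : _root_.List α) (k1 : α → κ₁) (k2 : α → κ₂) : Option α :=
  xs.foldl (fun acc x => match acc with
    | none => some x
    | some m => if k1 x < k1 m || (!(k1 m < k1 x) && k2 x < k2 m) then some x else some m) none
def max2? {κ₁ κ₂ : Type} [LT κ₁] [DecidableLT κ₁] [LT κ₂] [DecidableLT κ₂] (xs : _root_.List α) (k1 : α → κ₁) (k2 : α → κ₂) : Option α :=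
  xs.foldl (fun acc x => match acc with
    | none => some x
    | some m => if k1 m < k1 x || (!(k1 x < k1 m) && k2 m < k2 x) then some x else some m) none
theorem sorted2_perm {κ₁ κ₂ : Type} [LT κ₁] [DecidableLT κ₁] [LT κ₂] [DecidableLT κ₂] (xs : _root_.List α) (k1 : α → κ₁) (k2 : α → κ₂) (rev : Bool) :
    (sorted2 xs k1 k2 rev).Perm xs := by
  unfold sorted2; simpa using foldl_insertBy_perm _ xs []
@[simp] theorem length_sorted {κ : Type} [LT κ] [DecidableLT κ] (xs : _root_.List α) (key : α → κ) (rev : Bool) : (sorted xs key rev).length = xs.length :=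
  (sorted_perm xs key rev).length_eq

/-- Python `min(xs, key=key)`: the FIRST element whose key is minimal; `none` = ValueError on []. -/
def min? {κ : Type} [LT κ] [DecidableLT κ] (xs : _root_.List α) (key : α → κ) : Option α :=
  xs.foldl (fun acc x => match acc with | none => some x | some m => if key x < key m then some x else some m) none
/-- Python `max(xs, key=key)`: the FIRST element whose key is maximal; `none` = ValueError on []. -/
def max? {κ : Type} [LT κ] [DecidableLT κ] (xs : _root_.List α) (key : α → κ) : Option α :=
  xs.foldl (fun acc x => match acc with | none => some x | some m => if key m < key x then some x else some m) none

/-- Python `xs * n` / `n * xs`. -/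
def pyRepeat (xs : _root_.List α) (n : _root_.Int) : _root_.List α :=
  (_root_.List.replicate n.toNat xs).flatten

/-- Python `len(xs)` as an Int (Python ints are unbounded; a port compares it with Int-valued indices). -/
def len (xs : _root_.List α) : _root_.Int := xs.length

-- ---- bridge lemmas the ports' proofs keep needing (indexing by a natural, the last element, repeat, pop)
@[simp] theorem len_eq (xs : _root_.List α) : len xs = xs.length := rfl
theorem pyGet?_ofNat (xs : _root_.List α) (n : Nat) (h : n < xs.length) : pyGet? xs (n : _root_.Int) = some xs[n] := by
  rw [pyGet?_of_nonneg_of_lt xs (by omega) (by exact_mod_cast h)]; simp [h]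
@[simp] theorem pyGet?_zero_cons (x : α) (xs : _root_.List α) : pyGet? (x :: xs) 0 = some x := by
  simp [pyGet?, pyIdx?]
theorem pyGet?_neg_one (xs : _root_.List α) : pyGet? xs (-1) = xs.getLast? := by
  by_cases h : xs = []
  · subst h; simp [pyGet?, pyIdx?]
  have hl : 0 < xs.length := _root_.List.length_pos_iff.mpr h
  rw [pyGet?_neg xs (by omega) (by omega), _root_.List.getLast?_eq_getElem?]
  congr 1
theorem pyGet?_eq_getElem?_toNat (xs : _root_.List α) {i : _root_.Int} (h0 : 0 ≤ i) : pyGet? xs i = if i < xs.length then xs[i.toNat]? else none := by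
  split
  · exact pyGet?_of_nonneg_of_lt xs h0 (by assumption)
  · exact (pyGet?_eq_none_iff xs i).mpr (fun ⟨_, h2⟩ => by omega)
@[simp] theorem pyRepeat_singleton (a : α) (n : _root_.Int) : pyRepeat [a] n = _root_.List.replicate n.toNat a := by
  simp [pyRepeat]
@[simp] theorem pop?_zero_cons (x : α) (xs : _root_.List α) : pop? (x :: xs) 0 = some (x, xs) := by
  simp [pop?, pyIdx?]
theorem pop?_last (xs : _root_.List α) (x : α) : pop? (xs ++ [x]) (-1) = some (x, xs) := by
  have h : (1 : _root_.Int) ≤ (xs.length : _root_.Int) + 1 := by omega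
  simp [pop?, pyIdx?, h, _root_.List.eraseIdx_append_of_length_le]
@[simp] theorem length_slice_le (xs : _root_.List α) (a? b? : Option _root_.Int) : (slice xs a? b?).length ≤ xs.length := by
  simp [slice]; omega
@[simp] theorem mem_pyRange_one {a b x : _root_.Int} : x ∈ pyRange a b 1 ↔ a ≤ x ∧ x < b := by
  simp [pyRange_one, _root_.List.mem_map, _root_.List.mem_range]
  constructor
  · rintro ⟨k, hk, rfl⟩; omega
  · intro h; exact ⟨(x - a).toNat, by omega, by omega⟩
theorem pyRange_zero_nat (n : Nat) : pyRange 0 n 1 = (_root_.List.range n).map fun (k : Nat) => (k : _root_.Int) := by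
  simp [pyRange_zero]
/-- `range(a, b)` is empty when b ≤ a. -/
@[simp] theorem pyRange_one_eq_nil {a b : _root_.Int} (h : b ≤ a) : pyRange a b 1 = [] := by
  have : (b - a).toNat = 0 := by omega
  simp [pyRange_one, this]
/-- `range(a, b)` unrolled once from the left (the induction-friendly form): a :: range(a+1, b) when a < b. -/
theorem pyRange_one_cons {a b : _root_.Int} (h : a < b) : pyRange a b 1 = a :: pyRange (a + 1) b 1 := by
  rw [pyRange_one, pyRange_one]
  have hn : (b - a).toNat = (b - (a + 1)).toNat + 1 := by omega
  rw [hn, _root_.List.range_succ_eq_map]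
  simp [_root_.List.map_map, Function.comp_def]
  intro k _; omega
@[simp] theorem pyRange_one_singleton (a : _root_.Int) : pyRange a (a + 1) 1 = [a] := by
  rw [pyRange_one_cons (by omega), pyRange_one_eq_nil (by omega)]
/-- `range(a, b)` unrolled once from the right: range(a, b) ++ [b] = range(a, b+1) when a ≤ b. -/
theorem pyRange_one_succ_right {a b : _root_.Int} (h : a ≤ b) : pyRange a (b + 1) 1 = pyRange a b 1 ++ [b] := by
  rw [pyRange_one, pyRange_one]
  have hn : (b + 1 - a).toNat = (b - a).toNat + 1 := by omega
  rw [hn, _root_.List.range_succ, _root_.List.map_append]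
  simp; omega

/-- `xs[i]` with a default, at an in-range natural index, is the element. -/
theorem pyGetD_ofNat (xs : _root_.List α) (n : Nat) (d : α) (h : n < xs.length) : pyGetD xs (n : _root_.Int) d = xs[n] := by
  simp [pyGetD, pyGet?_ofNat xs n h]
theorem pyGetD_of_none (xs : _root_.List α) (i : _root_.Int) (d : α) (h : pyGet? xs i = none) : pyGetD xs i d = d := by
  simp [pyGetD, h]

/-- `xs.index(v)` (as Option Nat = core's idxOf?) fails exactly when v is absent. -/
theorem index?_eq_none_iff [BEq α] [LawfulBEq α] (xs : _root_.List α) (v : α) : index? xs v = none ↔ v ∉ xs := by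
  simp [index?]
@[simp] theorem index?_eq_idxOf? [BEq α] (xs : _root_.List α) (v : α) : index? xs v = xs.idxOf? v := rfl

/-- `xs.count(v)` is core's count. -/
@[simp] theorem count_eq [BEq α] (xs : _root_.List α) (v : α) : count xs v = xs.count v := rfl

theorem insertBy_mem_iff (before : α → α → Bool) (x y : α) (ys : _root_.List α) : y ∈ insertBy before x ys ↔ y = x ∨ y ∈ ys :=
  (insertBy_perm before x ys).mem_iff.trans (by simp)
@[simp] theorem mem_sorted {κ : Type} [LT κ] [DecidableLT κ] (xs : _root_.List α) (key : α → κ) (rev : Bool) (x : α) :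
    x ∈ sorted xs key rev ↔ x ∈ xs := (sorted_perm xs key rev).mem_iff

/-- `min(xs, key=…)` / `max` return a member of the list (none exactly on []). -/
private theorem foldl_pick_mem (pick : α → α → Bool) :
    ∀ (l : _root_.List α) (acc : Option α) (r : α),
      l.foldl (fun acc x => match acc with | none => some x | some m => if pick x m then some x else some m) acc = some r →
      r ∈ l ∨ acc = some r
  | [], acc, r, h => Or.inr (by simpa using h)
  | y :: ys, acc, r, h => by
    simp only [_root_.List.foldl_cons] at h
    rcases foldl_pick_mem pick ys _ r h with h1 | h1
    · exact Or.inl (_root_.List.mem_cons_of_mem _ h1)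
    · cases acc with
      | none =>
        have : y = r := by simpa using h1
        exact Or.inl (this ▸ _root_.List.mem_cons_self)
      | some a =>
        by_cases hp : pick y a = true
        · have : y = r := by simpa [hp] using h1
          exact Or.inl (this ▸ _root_.List.mem_cons_self)
        · have : a = r := by simpa [hp] using h1
          exact Or.inr (by simp [this])
/-- `min(xs, key=…)` / `max(…)` return a member of the list. -/
theorem min?_mem {κ : Type} [LT κ] [DecidableLT κ] {xs : _root_.List α} {key : α → κ} {m : α} (h : min? xs key = some m) : m ∈ xs := by
  rcases foldl_pick_mem (fun x m => decide (key x < key m)) xs none m (by simpa [min?] using h) with h' | h'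
  · exact h'
  · simp at h'
theorem max?_mem {κ : Type} [LT κ] [DecidableLT κ] {xs : _root_.List α} {key : α → κ} {m : α} (h : max? xs key = some m) : m ∈ xs := by
  rcases foldl_pick_mem (fun x m => decide (key m < key x)) xs none m (by simpa [max?] using h) with h' | h'
  · exact h'
  · simp at h'
@[simp] theorem min?_eq_none_iff {κ : Type} [LT κ] [DecidableLT κ] (xs : _root_.List α) (key : α → κ) : min? xs key = none ↔ xs = [] := by
  constructor
  · intro h; cases xs with
    | nil => rfl
    | cons y ys =>
      exfalso; unfold min? at h
      suffices H : ∀ (a : α) (l : _root_.List α), l.foldl (fun acc x => match acc with | none => some x | some m => if key x < key m then some x else some m) (some a) ≠ none by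
        exact H y ys (by simpa using h)
      intro a l; induction l generalizing a with
      | nil => simp
      | cons z zs ih => simp only [_root_.List.foldl_cons]; split <;> exact ih _
  · rintro rfl; rfl
@[simp] theorem max?_eq_none_iff {κ : Type} [LT κ] [DecidableLT κ] (xs : _root_.List α) (key : α → κ) : max? xs key = none ↔ xs = [] := by
  constructor
  · intro h; cases xs with
    | nil => rfl
    | cons y ys =>
      exfalso; unfold max? at h
      suffices H : ∀ (a : α) (l : _root_.List α), l.foldl (fun acc x => match acc with | none => some x | some m => if key m < key x then some x else some m) (some a) ≠ none by
        exact H y ys (by simpa using h)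
      intro a l; induction l generalizing a with
      | nil => simp
      | cons z zs ih => simp only [_root_.List.foldl_cons]; split <;> exact ih _
  · rintro rfl; rfl

/-- `xs.remove(v)` fails exactly when v is absent; otherwise the result is xs with its first v erased. -/
theorem remove?_eq_none_iff [BEq α] [LawfulBEq α] (xs : _root_.List α) (v : α) : remove? xs v = none ↔ v ∉ xs := by
  simp [remove?]

@[simp] theorem length_insert (xs : _root_.List α) (i : _root_.Int) (v : α) : (insert xs i v).length = xs.length + 1 := by
  simp [insert]; omega


/-! ### Lemma pack 3 — loop shapes. A Python 'for' loop ported as 'List.foldl' with an accumulator: the closed forms below turn the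
fold into map / filter / flatMap / count / sum, so a proof never re-derives them by induction. -/
section FoldShapes
variable {β γ δ : Type}

/-- 'out = acc; for x in l: out.append(f(x))' is acc ++ map f l. -/
theorem foldl_append_singleton_eq_map (f : α → β) (l : _root_.List α) (acc : _root_.List β) :
    l.foldl (fun acc x => acc ++ [f x]) acc = acc ++ l.map f := by
  induction l generalizing acc with
  | nil => simp
  | cons x t ih => simp [ih]
/-- 'for x in l: acc.append(x)' (copy loop). -/
theorem foldl_append_singleton_eq_self (l acc : _root_.List α) :
    l.foldl (fun acc x => acc ++ [x]) acc = acc ++ l := by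
  induction l generalizing acc with
  | nil => simp
  | cons x t ih => simp [ih]
/-- 'for x in l: if p(x): out.append(f(x))' is acc ++ (filter p l).map f  (Bool test). -/
theorem foldl_append_if (p : α → Bool) (f : α → β) (l : _root_.List α) (acc : _root_.List β) :
    l.foldl (fun acc x => if p x then acc ++ [f x] else acc) acc = acc ++ (l.filter p).map f := by
  induction l generalizing acc with
  | nil => simp
  | cons x t ih => cases hp : p x <;> simp [hp, ih]
/-- the same with a Prop test ('if x ∈ seen then …', 'if a < b then …'). -/
theorem foldl_append_ite (p : α → Prop) [DecidablePred p] (f : α → β) (l : _root_.List α) (acc : _root_.List β) :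
    l.foldl (fun acc x => if p x then acc ++ [f x] else acc) acc = acc ++ (l.filter (fun x => decide (p x))).map f := by
  induction l generalizing acc with
  | nil => simp
  | cons x t ih => by_cases hp : p x <;> simp [hp, ih]
/-- 'for x in l: if p(x): out.append(x)' is acc ++ filter p l. -/
theorem foldl_append_if_eq_filter (p : α → Bool) (l acc : _root_.List α) :
    l.foldl (fun acc x => if p x then acc ++ [x] else acc) acc = acc ++ l.filter p := by
  induction l generalizing acc with
  | nil => simp
  | cons x t ih => cases hp : p x <;> simp [hp, ih]
theorem foldl_append_ite_eq_filter (p : α → Prop) [DecidablePred p] (l acc : _root_.List α) :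
    l.foldl (fun acc x => if p x then acc ++ [x] else acc) acc = acc ++ l.filter (fun x => decide (p x)) := by
  induction l generalizing acc with
  | nil => simp
  | cons x t ih => by_cases hp : p x <;> simp [hp, ih]
/-- 'for x in l: out.extend(g(x))' / 'out += g(x)' is acc ++ flatMap g l. -/
theorem foldl_append_eq_flatMap (g : α → _root_.List β) (l : _root_.List α) (acc : _root_.List β) :
    l.foldl (fun acc x => acc ++ g x) acc = acc ++ l.flatMap g := by
  induction l generalizing acc with
  | nil => simp
  | cons x t ih => simp [ih]
/-- 'for chunk in xs: out += chunk' is acc ++ flatten xs. -/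
theorem foldl_append_eq_flatten (xs : _root_.List (_root_.List α)) (acc : _root_.List α) :
    xs.foldl (fun acc x => acc ++ x) acc = acc ++ xs.flatten := by
  induction xs generalizing acc with
  | nil => simp
  | cons x t ih => simp [ih]
/-- a loop body that only acts when p(x) holds is the loop over filter p l. -/
theorem foldl_if_eq_foldl_filter (p : α → Bool) (f : δ → α → δ) (l : _root_.List α) (init : δ) :
    l.foldl (fun acc x => if p x then f acc x else acc) init = (l.filter p).foldl f init := by
  induction l generalizing init with
  | nil => simp
  | cons x t ih => cases hp : p x <;> simp [hp, ih]
theorem foldl_ite_eq_foldl_filter (p : α → Prop) [DecidablePred p] (f : δ → α → δ) (l : _root_.List α) (init : δ) :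
    l.foldl (fun acc x => if p x then f acc x else acc) init = (l.filter (fun x => decide (p x))).foldl f init := by
  induction l generalizing init with
  | nil => simp
  | cons x t ih => by_cases hp : p x <;> simp [hp, ih]
/-- two loop bodies that agree on the list's elements give the same fold (rewrite INSIDE a ported loop). -/
theorem foldl_congr_mem (l : _root_.List α) (f g : β → α → β) (init : β) (h : ∀ acc x, x ∈ l → f acc x = g acc x) :
    l.foldl f init = l.foldl g init := by
  induction l generalizing init with
  | nil => rfl
  | cons x t ih =>
    simp only [_root_.List.foldl_cons]
    rw [h init x _root_.List.mem_cons_self]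
    exact ih _ (fun acc y hy => h acc y (_root_.List.mem_cons_of_mem _ hy))
/-- the same with the hypothesis in the other common order. -/
theorem foldl_congr_mem' (l : _root_.List α) (f g : β → α → β) (init : β) (h : ∀ x ∈ l, ∀ acc, f acc x = g acc x) :
    l.foldl f init = l.foldl g init :=
  foldl_congr_mem l f g init (fun acc x hx => h x hx acc)
/-- 'total = a; for x in l: total += g(x)' is a + sum (map g l)  (Int accumulator). -/
theorem foldl_add (l : _root_.List β) (g : β → _root_.Int) (a : _root_.Int) :
    l.foldl (fun acc x => acc + g x) a = a + (l.map g).sum := by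
  induction l generalizing a with
  | nil => simp
  | cons x t ih => simp [ih, Int.add_assoc]
theorem foldl_add_nat (l : _root_.List β) (g : β → Nat) (a : Nat) :
    l.foldl (fun acc x => acc + g x) a = a + (l.map g).sum := by
  induction l generalizing a with
  | nil => simp
  | cons x t ih => simp [ih, Nat.add_assoc]
/-- 'n = a; for x in l: if p(x): n += 1' is a + countP p l. -/
theorem foldl_if_add_one (p : α → Bool) (l : _root_.List α) (a : _root_.Int) :
    l.foldl (fun acc x => if p x then acc + 1 else acc) a = a + (l.countP p : _root_.Int) := by
  induction l generalizing a with
  | nil => simp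
  | cons x t ih => cases hp : p x <;> simp [hp, ih] <;> omega
theorem foldl_ite_add_one (p : α → Prop) [DecidablePred p] (l : _root_.List α) (a : _root_.Int) :
    l.foldl (fun acc x => if p x then acc + 1 else acc) a = a + (l.countP (fun x => decide (p x)) : _root_.Int) := by
  induction l generalizing a with
  | nil => simp
  | cons x t ih => by_cases hp : p x <;> simp [hp, ih] <;> omega
/-- 'for x in l: if x == v: n += 1' is a + l.count(v). -/
theorem foldl_beq_add_one [BEq α] (l : _root_.List α) (v : α) (a : _root_.Int) :
    l.foldl (fun acc x => if x == v then acc + 1 else acc) a = a + (l.count v : _root_.Int) := by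
  rw [foldl_if_add_one]; simp [_root_.List.count_eq_countP]
/-- a found-flag loop: 'ok = b; for x in l: if p(x): ok = False' is b && !any p l. -/
theorem foldl_if_false_eq (p : α → Bool) (l : _root_.List α) (b : Bool) :
    l.foldl (fun ok x => if p x then false else ok) b = (b && !l.any p) := by
  induction l generalizing b with
  | nil => simp
  | cons x t ih => rw [_root_.List.foldl_cons, ih]; cases hp : p x <;> cases b <;> simp [hp]
/-- 'found = b; for x in l: if p(x): found = True' is b || any p l. -/
theorem foldl_if_true_eq (p : α → Bool) (l : _root_.List α) (b : Bool) :
    l.foldl (fun ok x => if p x then true else ok) b = (b || l.any p) := by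
  induction l generalizing b with
  | nil => simp
  | cons x t ih => rw [_root_.List.foldl_cons, ih]; cases hp : p x <;> cases b <;> simp [hp]
theorem foldl_ite_false_eq (p : α → Prop) [DecidablePred p] (l : _root_.List α) (b : Bool) :
    l.foldl (fun ok x => if p x then false else ok) b = (b && !l.any (fun x => decide (p x))) := by
  induction l generalizing b with
  | nil => simp
  | cons x t ih => rw [_root_.List.foldl_cons, ih]; by_cases hp : p x <;> cases b <;> simp [hp]
theorem foldl_ite_true_eq (p : α → Prop) [DecidablePred p] (l : _root_.List α) (b : Bool) :
    l.foldl (fun ok x => if p x then true else ok) b = (b || l.any (fun x => decide (p x))) := by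
  induction l generalizing b with
  | nil => simp
  | cons x t ih => rw [_root_.List.foldl_cons, ih]; by_cases hp : p x <;> cases b <;> simp [hp]
/-- a loop that never changes its accumulator. -/
@[simp] theorem foldl_ignore (l : _root_.List α) (init : β) : l.foldl (fun acc _ => acc) init = init := by
  induction l <;> simp_all

end FoldShapes

/-! ### Lemma pack 3 — indexing / slicing / range bridge lemmas at NATURAL indices (the common case after 'for i in range(len(xs))'). -/

/-- xs[n] at a natural index is core's xs[n]? outright (none past the end on both sides). -/
@[simp] theorem pyGet?_natCast (xs : _root_.List α) (n : Nat) : pyGet? xs (n : _root_.Int) = xs[n]? := by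
  by_cases h : n < xs.length
  · rw [pyGet?_ofNat xs n h]; simp [h]
  · rw [(pyGet?_eq_none_iff xs n).mpr (fun ⟨_, h2⟩ => h (by exact_mod_cast h2))]; simp [_root_.List.getElem?_eq_none (Nat.le_of_not_lt h)]
/-- xs[i] for 0 ≤ i is xs[i.toNat]? (none past the end on both sides). -/
theorem pyGet?_of_nonneg (xs : _root_.List α) {i : _root_.Int} (h : 0 ≤ i) : pyGet? xs i = xs[i.toNat]? := by
  obtain ⟨n, rfl⟩ := Int.eq_ofNat_of_zero_le h
  rw [pyGet?_natCast]; simp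
@[simp] theorem pyGetD_natCast (xs : _root_.List α) (n : Nat) (d : α) : pyGetD xs (n : _root_.Int) d = xs.getD n d := by
  simp [pyGetD, _root_.List.getD_eq_getElem?_getD]
theorem pyGetD_eq_getElem (xs : _root_.List α) {i : _root_.Int} (d : α) (h0 : 0 ≤ i) (h1 : i < xs.length) :
    pyGetD xs i d = xs[i.toNat]'(by omega) := by
  simp [pyGetD, pyGet?_of_nonneg xs h0, _root_.List.getElem?_eq_getElem (show i.toNat < xs.length by omega)]
/-- xs[n+1] of a cons is xs-tail[n]. -/
@[simp] theorem pyGet?_cons_succ (x : α) (xs : _root_.List α) (n : Nat) : pyGet? (x :: xs) ((n : _root_.Int) + 1) = pyGet? xs n := by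
  rw [show ((n : _root_.Int) + 1) = ((n + 1 : Nat) : _root_.Int) by simp, pyGet?_natCast, pyGet?_natCast]; simp
/-- (pre ++ ys)[len(pre) + k] is ys[k]. -/
theorem pyGet?_append_right (pre ys : _root_.List α) (k : Nat) : pyGet? (pre ++ ys) ((pre.length : _root_.Int) + k) = ys[k]? := by
  rw [show ((pre.length : _root_.Int) + k) = ((pre.length + k : Nat) : _root_.Int) by simp, pyGet?_natCast,
    _root_.List.getElem?_append_right (by omega)]; simp
theorem pyGet?_append_length (pre ys : _root_.List α) (y : α) : pyGet? (pre ++ y :: ys) (pre.length : _root_.Int) = some y := by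
  rw [pyGet?_natCast, _root_.List.getElem?_append_right (by omega)]; simp
/-- xs[-k] for 0 < k ≤ len is the element k from the end. -/
theorem pyGet?_neg_natCast (xs : _root_.List α) (k : Nat) (hk : 0 < k) (hk' : k ≤ xs.length) :
    pyGet? xs (-(k : _root_.Int)) = xs[xs.length - k]? := by
  rw [pyGet?_neg xs (by omega) (by omega)]; congr 1; omega
theorem pyGetD_neg_natCast (xs : _root_.List α) (k : Nat) (d : α) (hk : 0 < k) (hk' : k ≤ xs.length) :
    pyGetD xs (-(k : _root_.Int)) d = xs[xs.length - k]'(by omega) := by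
  simp [pyGetD, pyGet?_neg_natCast xs k hk hk', _root_.List.getElem?_eq_getElem (show xs.length - k < xs.length by omega)]
/-- the element Python reads is a member of the list. -/
theorem mem_of_pyGet?_eq_some (xs : _root_.List α) {i : _root_.Int} {x : α} (h : pyGet? xs i = some x) : x ∈ xs := by
  unfold pyGet? at h
  cases hk : pyIdx? xs.length i with
  | none => simp [hk] at h
  | some k => simp only [hk, Option.bind_some] at h; exact _root_.List.mem_of_getElem? h
theorem pyGetD_mem (xs : _root_.List α) {i : _root_.Int} (d : α) (h : Raise.InRange xs.length i) : pyGetD xs i d ∈ xs := by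
  cases hg : pyGet? xs i with
  | none => exact absurd ((pyGet?_eq_none_iff xs i).mp hg) (fun hn => hn h)
  | some x => simp [pyGetD, hg]; exact mem_of_pyGet?_eq_some xs hg
/-- xs[n] = v at a natural index in range is core's set. -/
@[simp] theorem pySet?_natCast (xs : _root_.List α) (n : Nat) (v : α) (h : n < xs.length) : pySet? xs (n : _root_.Int) v = some (xs.set n v) := by
  simp [pySet?, pyIdx?, h]
theorem pySet?_eq_none_iff (xs : _root_.List α) (i : _root_.Int) (v : α) : pySet? xs i v = none ↔ ¬ Raise.InRange xs.length i := by
  simp only [pySet?, pyIdx?, Raise.InRange]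
  split <;> split <;> simp <;> omega
/-- Python xs[i] = v kept total: the list unchanged where Python would raise — ONLY for ports whose Pre_ states Raise.InRange xs.length i. -/
def pySetD (xs : _root_.List α) (i : _root_.Int) (v : α) : _root_.List α := (pySet? xs i v).getD xs
/-- at a natural index pySetD is core's List.set outright (both leave the list alone past the end). -/
@[simp] theorem pySetD_natCast (xs : _root_.List α) (n : Nat) (v : α) : pySetD xs (n : _root_.Int) v = xs.set n v := by
  by_cases h : n < xs.length
  · simp [pySetD, h]
  · have : pySet? xs (n : _root_.Int) v = none := (pySet?_eq_none_iff xs n v).mpr (fun ⟨_, h2⟩ => h (by exact_mod_cast h2))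
    simp [pySetD, this, _root_.List.set_eq_of_length_le (Nat.le_of_not_lt h)]
@[simp] theorem length_pySetD (xs : _root_.List α) (i : _root_.Int) (v : α) : (pySetD xs i v).length = xs.length := by
  unfold pySetD pySet?; cases pyIdx? xs.length i <;> simp
theorem pyGetD_pySetD_natCast (xs : _root_.List α) (n m : Nat) (v d : α) (hn : n < xs.length) :
    pyGetD (pySetD xs n v) m d = if m = n then v else pyGetD xs m d := by
  simp only [pySetD_natCast, pyGetD_natCast, _root_.List.getD_eq_getElem?_getD]
  by_cases h : m = n
  · subst h; simp [hn]
  · rw [_root_.List.getElem?_set_ne (Ne.symm h)]; simp [h]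

/-- xs.pop(n) at an in-range natural index. -/
theorem pop?_natCast (xs : _root_.List α) (n : Nat) (h : n < xs.length) : pop? xs (n : _root_.Int) = some (xs[n], xs.eraseIdx n) := by
  simp [pop?, pyIdx?, h]
theorem length_of_pop?_eq_some (xs : _root_.List α) {i : _root_.Int} {r : α × _root_.List α} (h : pop? xs i = some r) : r.2.length + 1 = xs.length := by
  unfold pop? at h
  cases hk : pyIdx? xs.length i with
  | none => simp [hk] at h
  | some k =>
    simp only [hk, Option.bind_some] at h
    cases hx : xs[k]? with
    | none => simp [hx] at h
    | some x =>
      simp only [hx, Option.map_some, Option.some.injEq] at h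
      subst h
      have hk' : k < xs.length := (_root_.List.getElem?_eq_some_iff.mp hx).1
      simp [_root_.List.length_eraseIdx, hk']; omega
/-- xs.remove(v) when v is the head / is not the head. -/
@[simp] theorem remove?_cons_self [BEq α] [LawfulBEq α] (x : α) (xs : _root_.List α) : remove? (x :: xs) x = some xs := by
  simp [remove?, _root_.List.idxOf?_cons]
theorem remove?_cons_of_ne [BEq α] [LawfulBEq α] {x v : α} (xs : _root_.List α) (h : x ≠ v) :
    remove? (x :: xs) v = (remove? xs v).map (fun t => x :: t) := by
  have hb : (x == v) = false := by simpa [beq_iff_eq] using h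
  simp [remove?, _root_.List.idxOf?_cons, hb, Option.map_map, Function.comp_def]
/-- xs.remove(v) for a present v is core's erase (first occurrence). -/
theorem remove?_eq_some_erase [BEq α] [LawfulBEq α] (xs : _root_.List α) (v : α) (h : v ∈ xs) : remove? xs v = some (xs.erase v) := by
  induction xs with
  | nil => simp at h
  | cons x t ih =>
    by_cases hx : x = v
    · subst hx; simp
    · rw [remove?_cons_of_ne t hx, _root_.List.erase_cons_tail (by simpa [beq_iff_eq] using hx)]
      have : v ∈ t := by simpa [Ne.symm hx] using h
      simp [ih this]
/-- xs.index(v) on a cons: found at the head, or one past where the tail finds it. -/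
theorem index?_cons_self [BEq α] [LawfulBEq α] (x : α) (xs : _root_.List α) : index? (x :: xs) x = some 0 := by
  simp [index?, _root_.List.idxOf?_cons]
theorem index?_cons_of_ne [BEq α] [LawfulBEq α] {x v : α} (xs : _root_.List α) (h : x ≠ v) : index? (x :: xs) v = (index? xs v).map (· + 1) := by
  have hb : (x == v) = false := by simpa [beq_iff_eq] using h
  simp [index?, _root_.List.idxOf?_cons, hb]
/-- l + [c] . index(c) for a fresh c is len(l). -/
theorem index?_append_singleton_self [BEq α] [LawfulBEq α] (l : _root_.List α) (c : α) (h : c ∉ l) : index? (l ++ [c]) c = some l.length := by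
  induction l with
  | nil => simp
  | cons x t ih =>
    have hx : x ≠ c := fun e => h (e ▸ _root_.List.mem_cons_self)
    rw [_root_.List.cons_append, index?_cons_of_ne _ hx, ih (fun hm => h (_root_.List.mem_cons_of_mem _ hm))]; simp
theorem index?_isSome_iff [BEq α] [LawfulBEq α] (xs : _root_.List α) (v : α) : (index? xs v).isSome ↔ v ∈ xs := by
  rw [Option.isSome_iff_ne_none, ne_eq, index?_eq_none_iff]; simp

/-- an element of a slice is an element of the list. -/
theorem mem_of_mem_slice (xs : _root_.List α) (a? b? : Option _root_.Int) {x : α} (h : x ∈ slice xs a? b?) : x ∈ xs := by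
  simp only [slice] at h; exact _root_.List.mem_of_mem_drop (_root_.List.mem_of_mem_take h)
@[simp] theorem clampIdx_le (n : Nat) (i : _root_.Int) : clampIdx n i ≤ n := by
  unfold clampIdx; split <;> (try split) <;> omega
@[simp] theorem clampIdx_natCast (n k : Nat) : clampIdx n (k : _root_.Int) = min k n := by
  rw [clampIdx_of_nonneg (by omega)]; simp
/-- xs[a:b] at NATURAL bounds is drop/take outright — no side conditions (both sides clamp the same way). -/
theorem slice_natCast (xs : _root_.List α) (a b : Nat) : slice xs (some (a : _root_.Int)) (some (b : _root_.Int)) = (xs.drop a).take (b - a) := by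
  simp only [slice, clampIdx_natCast]
  by_cases ha : a ≤ xs.length
  · by_cases hb : b ≤ xs.length
    · rw [Nat.min_eq_left ha, Nat.min_eq_left hb]
    · rw [Nat.min_eq_left ha, Nat.min_eq_right (by omega), _root_.List.take_of_length_le (by simp),
        _root_.List.take_of_length_le (by simp; omega)]
  · have hn : xs.length ≤ a := by omega
    rw [Nat.min_eq_right hn, _root_.List.drop_of_length_le hn, _root_.List.drop_of_length_le (Nat.le_refl _)]; simp
/-- xs[j:j+n] at natural j, n is (drop j xs).take n. -/
theorem slice_natCast_add (xs : _root_.List α) (j n : Nat) :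
    slice xs (some (j : _root_.Int)) (some ((j : _root_.Int) + (n : _root_.Int))) = (xs.drop j).take n := by
  rw [show ((j : _root_.Int) + (n : _root_.Int)) = ((j + n : Nat) : _root_.Int) by simp, slice_natCast]; simp
/-- xs[:b] / xs[a:] at natural bounds. -/
@[simp] theorem slice_to_natCast (xs : _root_.List α) (b : Nat) : slice xs none (some (b : _root_.Int)) = xs.take b := by
  rw [slice_to xs (by omega)]; simp
@[simp] theorem slice_from_natCast (xs : _root_.List α) (a : Nat) : slice xs (some (a : _root_.Int)) none = xs.drop a := by
  rw [slice_from xs (by omega)]; simp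
/-- xs[0:b] is xs[:b] (a literal 0 start). -/
@[simp] theorem slice_zero_start (xs : _root_.List α) (b? : Option _root_.Int) : slice xs (some 0) b? = slice xs none b? := by
  simp [slice, clampIdx]
/-- xs[a:] for ANY a is a drop to the clamped position. -/
theorem slice_some_none (xs : _root_.List α) (a : _root_.Int) : slice xs (some a) none = xs.drop (clampIdx xs.length a) := by
  simp only [slice]; rw [_root_.List.take_of_length_le (by simp)]
/-- xs[:-k] / xs[-k:] for 0 < k ≤ len: all but the last k / the last k. -/
theorem slice_to_neg_natCast (xs : _root_.List α) (k : Nat) (hk : 0 < k) : slice xs none (some (-(k : _root_.Int))) = xs.take (xs.length - k) := by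
  simp only [slice]
  have : clampIdx xs.length (-(k : _root_.Int)) = xs.length - k := by unfold clampIdx; split <;> (try split) <;> omega
  simp [this]
theorem slice_from_neg_natCast (xs : _root_.List α) (k : Nat) (hk : 0 < k) : slice xs (some (-(k : _root_.Int))) none = xs.drop (xs.length - k) := by
  rw [slice_some_none]
  have : clampIdx xs.length (-(k : _root_.Int)) = xs.length - k := by unfold clampIdx; split <;> (try split) <;> omega
  rw [this]
/-- the length of any step-1 slice. -/
theorem length_slice (xs : _root_.List α) (a b : _root_.Int) :
    (slice xs (some a) (some b)).length = clampIdx xs.length b - clampIdx xs.length a := by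
  simp only [slice, _root_.List.length_take, _root_.List.length_drop]
  have := clampIdx_le xs.length b; omega

/-- range(a, b) split at an intermediate point: range(a, m) ++ range(m, b). -/
theorem pyRange_one_append (a m b : _root_.Int) (h1 : a ≤ m) (h2 : m ≤ b) : pyRange a b 1 = pyRange a m 1 ++ pyRange m b 1 := by
  rw [pyRange_one, pyRange_one, pyRange_one]
  have hn : (b - a).toNat = (m - a).toNat + (b - m).toNat := by omega
  rw [hn, _root_.List.range_add, _root_.List.map_append, _root_.List.map_map]
  congr 1
  apply _root_.List.map_congr_left; intro k hk; simp; omega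
/-- the k-th element of range(a, b) is a + k. -/
@[simp] theorem getElem?_pyRange_one (a b : _root_.Int) (k : Nat) : (pyRange a b 1)[k]? = if k < (b - a).toNat then some (a + k) else none := by
  rw [pyRange_one]; split
  · rw [_root_.List.getElem?_map, _root_.List.getElem?_range (by assumption)]; rfl
  · rw [_root_.List.getElem?_eq_none (by simp; omega)]
@[simp] theorem getElem_pyRange_one (a b : _root_.Int) (k : Nat) (h : k < (pyRange a b 1).length) : (pyRange a b 1)[k] = a + k := by
  apply Option.some.inj; rw [← _root_.List.getElem?_eq_getElem, getElem?_pyRange_one]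
  simp only [length_pyRange_one] at h; simp [h]
/-- range(a, b) is strictly increasing, hence duplicate-free. -/
theorem pairwise_lt_pyRange_one (a b : _root_.Int) : (pyRange a b 1).Pairwise (· < ·) := by
  rw [pyRange_one, _root_.List.pairwise_map]
  exact _root_.List.Pairwise.imp (fun h => by omega) _root_.List.pairwise_lt_range
theorem nodup_pyRange_one (a b : _root_.Int) : (pyRange a b 1).Nodup :=
  _root_.List.Pairwise.imp (fun h => by omega) (pairwise_lt_pyRange_one a b)
/-- range(a, b, -1): counting down, as an explicit map / by unrolling. -/
theorem pyRange_neg_one (a b : _root_.Int) : pyRange a b (-1) = (_root_.List.range (a - b).toNat).map fun (k : Nat) => a - (k : _root_.Int) := by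
  unfold pyRange
  have h1 : ¬ ((-1 : _root_.Int) = 0) := by decide
  have h2 : ¬ ((0 : _root_.Int) < -1) := by decide
  simp only [h1, h2, ↓reduceIte, Int.neg_neg, Int.ediv_one]
  by_cases h : b < a
  · simp only [h, ↓reduceIte]
    rw [show a - b + 1 - 1 = a - b by omega]
    apply _root_.List.map_congr_left; intro k _; omega
  · simp only [h, ↓reduceIte]
    have : (a - b).toNat = 0 := by omega
    rw [this]; rfl
@[simp] theorem pyRange_neg_one_eq_nil {a b : _root_.Int} (h : a ≤ b) : pyRange a b (-1) = [] := by
  have : (a - b).toNat = 0 := by omega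
  simp [pyRange_neg_one, this]
theorem pyRange_neg_one_cons {a b : _root_.Int} (h : b < a) : pyRange a b (-1) = a :: pyRange (a - 1) b (-1) := by
  rw [pyRange_neg_one, pyRange_neg_one]
  have hn : (a - b).toNat = (a - 1 - b).toNat + 1 := by omega
  rw [hn, _root_.List.range_succ_eq_map]
  simp [_root_.List.map_map, Function.comp_def]
  intro k _; omega
@[simp] theorem mem_pyRange_neg_one {a b x : _root_.Int} : x ∈ pyRange a b (-1) ↔ b < x ∧ x ≤ a := by
  simp [pyRange_neg_one, _root_.List.mem_map, _root_.List.mem_range]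
  constructor
  · rintro ⟨k, hk, rfl⟩; omega
  · intro h; exact ⟨(a - x).toNat, by omega, by omega⟩
@[simp] theorem length_pyRange_neg_one (a b : _root_.Int) : (pyRange a b (-1)).length = (a - b).toNat := by simp [pyRange_neg_one]
/-- range(a, b, -1) is range(b+1, a+1) reversed (the usual way to reason about a countdown). -/
theorem pyRange_neg_one_eq_reverse (a b : _root_.Int) : pyRange a b (-1) = (pyRange (b + 1) (a + 1) 1).reverse := by
  suffices H : ∀ (n : Nat) (a : _root_.Int), (a - b).toNat = n → pyRange a b (-1) = (pyRange (b + 1) (a + 1) 1).reverse from H _ a rfl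
  intro n
  induction n with
  | zero => intro a h; rw [pyRange_neg_one_eq_nil (by omega), pyRange_one_eq_nil (by omega)]; rfl
  | succ n ih =>
    intro a h
    rw [pyRange_neg_one_cons (by omega), ih (a - 1) (by omega), show a - 1 + 1 = a by omega,
      pyRange_one_succ_right (show b + 1 ≤ a by omega)]
    simp
/-- 'for i in range(a, len(xs)): … xs[i] …' reads exactly the elements of xs from position a on. -/
theorem map_pyGetD_pyRange (xs : _root_.List α) (d : α) {a : _root_.Int} (ha : 0 ≤ a) :
    (pyRange a (len xs) 1).map (fun j => pyGetD xs j d) = xs.drop a.toNat := by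
  apply _root_.List.ext_getElem?; intro i
  simp only [_root_.List.getElem?_map, getElem?_pyRange_one, len_eq, _root_.List.getElem?_drop]
  split
  · rename_i hi
    have e : a + (i : _root_.Int) = ((a.toNat + i : Nat) : _root_.Int) := by omega
    simp only [Option.map_some, e, pyGetD_natCast, _root_.List.getD_eq_getElem?_getD]
    rw [_root_.List.getElem?_eq_getElem (show a.toNat + i < xs.length by omega)]; simp
  · rw [Option.map_none, eq_comm, _root_.List.getElem?_eq_none (by omega)]
theorem map_pyGetD_pyRange_zero (xs : _root_.List α) (d : α) : (pyRange 0 (len xs) 1).map (fun j => pyGetD xs j d) = xs := by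
  simpa using map_pyGetD_pyRange xs d (Int.le_refl 0)
/-- the same two facts with the bound written '(xs.length : Int)' — the form 'simp' leaves (len_eq is @[simp]). -/
theorem map_pyGetD_pyRange' (xs : _root_.List α) (d : α) {a : _root_.Int} (ha : 0 ≤ a) :
    (pyRange a (xs.length : _root_.Int) 1).map (fun j => pyGetD xs j d) = xs.drop a.toNat := map_pyGetD_pyRange xs d ha
theorem map_pyGetD_pyRange_zero' (xs : _root_.List α) (d : α) : (pyRange 0 (xs.length : _root_.Int) 1).map (fun j => pyGetD xs j d) = xs :=
  map_pyGetD_pyRange_zero xs d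
/-- … so an index loop over range(a, len(xs)) is the element loop over xs[a:]. -/
theorem foldl_pyRange_pyGetD {β : Type} (xs : _root_.List α) (d : α) (f : β → α → β) (init : β) {a : _root_.Int} (ha : 0 ≤ a) :
    (pyRange a (len xs) 1).foldl (fun acc j => f acc (pyGetD xs j d)) init = (xs.drop a.toNat).foldl f init := by
  rw [← map_pyGetD_pyRange xs d ha, _root_.List.foldl_map]
theorem foldl_pyRange_zero_pyGetD {β : Type} (xs : _root_.List α) (d : α) (f : β → α → β) (init : β) :
    (pyRange 0 (len xs) 1).foldl (fun acc j => f acc (pyGetD xs j d)) init = xs.foldl f init := by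
  simpa using foldl_pyRange_pyGetD xs d f init (Int.le_refl 0)

theorem foldl_pyRange_pyGetD' {β : Type} (xs : _root_.List α) (d : α) (f : β → α → β) (init : β) {a : _root_.Int} (ha : 0 ≤ a) :
    (pyRange a (xs.length : _root_.Int) 1).foldl (fun acc j => f acc (pyGetD xs j d)) init = (xs.drop a.toNat).foldl f init :=
  foldl_pyRange_pyGetD xs d f init ha
theorem foldl_pyRange_zero_pyGetD' {β : Type} (xs : _root_.List α) (d : α) (f : β → α → β) (init : β) :
    (pyRange 0 (xs.length : _root_.Int) 1).foldl (fun acc j => f acc (pyGetD xs j d)) init = xs.foldl f init :=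
  foldl_pyRange_zero_pyGetD xs d f init

/-- Python 'enumerate(xs, start)': the pairs (index, element), index an Int counting from start. -/
def enumerate (xs : _root_.List α) (start : _root_.Int := 0) : _root_.List (_root_.Int × α) :=
  match xs with
  | [] => []
  | x :: t => (start, x) :: enumerate t (start + 1)
@[simp] theorem enumerate_nil (s : _root_.Int) : enumerate ([] : _root_.List α) s = [] := rfl
@[simp] theorem enumerate_cons (x : α) (xs : _root_.List α) (s : _root_.Int) : enumerate (x :: xs) s = (s, x) :: enumerate xs (s + 1) := rfl
@[simp] theorem length_enumerate (xs : _root_.List α) (s : _root_.Int) : (enumerate xs s).length = xs.length := by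
  induction xs generalizing s <;> simp_all [enumerate]
@[simp] theorem map_snd_enumerate (xs : _root_.List α) (s : _root_.Int) : (enumerate xs s).map (·.2) = xs := by
  induction xs generalizing s <;> simp_all
theorem map_fst_enumerate (xs : _root_.List α) (s : _root_.Int) : (enumerate xs s).map (·.1) = pyRange s (s + xs.length) 1 := by
  induction xs generalizing s with
  | nil => simp
  | cons x t ih =>
    rw [enumerate_cons, _root_.List.map_cons, ih, pyRange_one_cons (a := s) (by simp only [_root_.List.length_cons]; omega)]
    simp only [_root_.List.length_cons]
    rw [show s + 1 + (t.length : _root_.Int) = s + ((t.length + 1 : Nat) : _root_.Int) by omega]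
/-- enumerate as the familiar zipIdx, and element-wise. -/
theorem enumerate_eq_zipIdx_map (xs : _root_.List α) (s : _root_.Int) : enumerate xs s = (xs.zipIdx 0).map (fun p => (s + (p.2 : _root_.Int), p.1)) := by
  induction xs generalizing s with
  | nil => simp
  | cons x t ih =>
    rw [enumerate_cons, ih, _root_.List.zipIdx_cons, _root_.List.map_cons, _root_.List.zipIdx_succ, _root_.List.map_map]
    simp [Function.comp_def]; intro a b _; omega
@[simp] theorem getElem?_enumerate (xs : _root_.List α) (s : _root_.Int) (k : Nat) : (enumerate xs s)[k]? = xs[k]?.map (fun x => (s + k, x)) := by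
  induction xs generalizing s k with
  | nil => simp
  | cons x t ih => cases k with
    | zero => simp
    | succ k => simp [ih]; cases t[k]? <;> simp; omega
theorem getElem_enumerate (xs : _root_.List α) (s : _root_.Int) (k : Nat) (h : k < (enumerate xs s).length) :
    (enumerate xs s)[k] = (s + k, xs[k]'(by simpa using h)) := by
  apply Option.some.inj; rw [← _root_.List.getElem?_eq_getElem, getElem?_enumerate, _root_.List.getElem?_eq_getElem (by simpa using h)]; rfl
theorem mem_enumerate_iff (xs : _root_.List α) (s : _root_.Int) (p : _root_.Int × α) :
    p ∈ enumerate xs s ↔ ∃ (k : Nat) (h : k < xs.length), p = (s + k, xs[k]) := by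
  rw [_root_.List.mem_iff_getElem?]; simp only [getElem?_enumerate]
  constructor
  · rintro ⟨k, hk⟩
    cases hx : xs[k]? with
    | none => simp [hx] at hk
    | some x =>
      obtain ⟨hl, rfl⟩ := _root_.List.getElem?_eq_some_iff.mp hx
      simp [hx] at hk
      exact ⟨k, hl, hk.symm⟩
  · rintro ⟨k, hk, rfl⟩; exact ⟨k, by simp [_root_.List.getElem?_eq_getElem hk]⟩
/-- the indices of enumerate are strictly increasing (so the pairs are duplicate-free). -/
theorem pairwise_lt_enumerate (xs : _root_.List α) (s : _root_.Int) : (enumerate xs s).Pairwise (fun p q => p.1 < q.1) := by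
  have h := pairwise_lt_pyRange_one s (s + xs.length)
  rw [← map_fst_enumerate, _root_.List.pairwise_map] at h; exact h
theorem enumerate_append (xs ys : _root_.List α) (s : _root_.Int) : enumerate (xs ++ ys) s = enumerate xs s ++ enumerate ys (s + xs.length) := by
  induction xs generalizing s with
  | nil => simp
  | cons x t ih =>
    simp only [_root_.List.cons_append, enumerate_cons, ih, _root_.List.length_cons]
    rw [show s + 1 + (t.length : _root_.Int) = s + ((t.length + 1 : Nat) : _root_.Int) by omega]
/-- 'for i, x in enumerate(xs)' with a body that reads xs[i] reads x. -/
theorem enumerate_eq_map_pyRange (xs : _root_.List α) (d : α) : enumerate xs 0 = (pyRange 0 (len xs) 1).map (fun j => (j, pyGetD xs j d)) := by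
  apply _root_.List.ext_getElem?; intro i
  simp only [getElem?_enumerate, _root_.List.getElem?_map, getElem?_pyRange_one, len_eq]
  by_cases hi : i < xs.length
  · simp [hi, _root_.List.getD_eq_getElem?_getD]
  · simp [hi]

/-- alias in the conventional name: membership in one stable-insertion step. -/
theorem mem_insertBy (before : α → α → Bool) (x y : α) (ys : _root_.List α) : y ∈ insertBy before x ys ↔ y = x ∨ y ∈ ys :=
  insertBy_mem_iff before x y ys
theorem sorted_eq_nil_iff {κ : Type} [LT κ] [DecidableLT κ] (xs : _root_.List α) (key : α → κ) (rev : Bool) : sorted xs key rev = [] ↔ xs = [] := by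
  rw [← _root_.List.length_eq_zero_iff, length_sorted, _root_.List.length_eq_zero_iff]
theorem sorted_eq_foldl_insertBy {κ : Type} [LT κ] [DecidableLT κ] (xs : _root_.List α) (key : α → κ) :
    sorted xs key false = xs.foldl (fun acc x => insertBy (fun a b => decide (key a < key b)) x acc) [] := rfl
theorem sorted_rev_eq_foldl_insertBy {κ : Type} [LT κ] [DecidableLT κ] (xs : _root_.List α) (key : α → κ) :
    sorted xs key true = xs.foldl (fun acc x => insertBy (fun a b => decide (key b < key a)) x acc) [] := rfl
/-- an insertion step that finds nothing to precede appends (the key to 'sorted of an already-sorted list'). -/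
theorem insertBy_of_forall_not_before (before : α → α → Bool) (x : α) (ys : _root_.List α) (h : ∀ y ∈ ys, before x y = false) :
    insertBy before x ys = ys ++ [x] := by
  induction ys with
  | nil => rfl
  | cons y t ih => simp only [insertBy, h y _root_.List.mem_cons_self]; simp [ih (fun z hz => h z (_root_.List.mem_cons_of_mem _ hz))]

/-! ### Lemma pack 4 — numeral indices, xs[-1] / xs[0], comprehension-over-range indexing, s[::-1] and xs[:-1], list.index as a position, list.insert, two-accumulator loops, running max -/

/-- xs[-2], xs[-3], … with a NUMERAL index (the '_neg_natCast' lemmas match a cast '-(k : Int)', not a numeral). -/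
theorem pyGetD_neg_ofNat (xs : _root_.List α) (k : Nat) (d : α) (hk : 0 < k) (h : k ≤ xs.length) :
    pyGetD xs (-(no_index (OfNat.ofNat k) : _root_.Int)) d = xs[xs.length - k]'(by omega) :=
  pyGetD_neg_natCast xs k d hk h
theorem pyGet?_neg_ofNat (xs : _root_.List α) (k : Nat) (hk : 0 < k) (h : k ≤ xs.length) :
    pyGet? xs (-(no_index (OfNat.ofNat k) : _root_.Int)) = xs[xs.length - k]? :=
  pyGet?_neg_natCast xs k hk h
/-- xs[:-2] / xs[-2:] … with a NUMERAL bound ≥ 2 (xs[:-1] is slice_to_neg_one = dropLast, xs[-1:] is slice_from_neg_one). -/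
theorem slice_to_neg_ofNat (xs : _root_.List α) (k : Nat) (hk : 1 < k) :
    slice xs none (some (-(no_index (OfNat.ofNat k) : _root_.Int))) = xs.take (xs.length - k) :=
  slice_to_neg_natCast xs k (by omega)
theorem slice_from_neg_ofNat (xs : _root_.List α) (k : Nat) (hk : 1 < k) :
    slice xs (some (-(no_index (OfNat.ofNat k) : _root_.Int))) none = xs.drop (xs.length - k) :=
  slice_from_neg_natCast xs k (by omega)
/-- the clamped position a negative bound -k denotes is len - k (truncated at 0), so 'slice_some_none' output normalises. -/
@[simp] theorem clampIdx_neg_natCast (n k : Nat) (hk : 0 < k) : clampIdx n (-(k : _root_.Int)) = n - k := by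
  unfold clampIdx; split <;> (try split) <;> omega
@[simp] theorem clampIdx_neg_ofNat (n k : Nat) (hk : 0 < k) : clampIdx n (-(no_index (OfNat.ofNat k) : _root_.Int)) = n - k :=
  clampIdx_neg_natCast n k hk
@[simp] theorem clampIdx_neg_one (n : Nat) : clampIdx n (-1) = n - 1 := clampIdx_neg_natCast n 1 (by omega)

/-- xs[-1] under Pre_ 'xs ≠ []' is the last element. -/
theorem pyGetD_neg_one (xs : _root_.List α) (d : α) (h : xs ≠ []) : pyGetD xs (-1) d = xs.getLast h := by
  simp [pyGetD, pyGet?_neg_one, _root_.List.getLast?_eq_some_getLast h]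
@[simp] theorem pyGet?_neg_one_append_singleton (xs : _root_.List α) (x : α) : pyGet? (xs ++ [x]) (-1) = some x := by
  simp [pyGet?_neg_one]
@[simp] theorem pyGetD_neg_one_append_singleton (xs : _root_.List α) (x d : α) : pyGetD (xs ++ [x]) (-1) d = x := by
  simp [pyGetD]
/-- xs[0] of a cons / xs[0] in general. -/
@[simp] theorem pyGetD_zero_cons (x : α) (xs : _root_.List α) (d : α) : pyGetD (x :: xs) 0 d = x := by simp [pyGetD]
theorem pyGet?_zero (xs : _root_.List α) : pyGet? xs 0 = xs[0]? := by
  rw [show (0 : _root_.Int) = ((0 : Nat) : _root_.Int) by rfl, pyGet?_natCast]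
theorem pyGetD_zero (xs : _root_.List α) (d : α) : pyGetD xs 0 d = xs.getD 0 d := by
  rw [show (0 : _root_.Int) = ((0 : Nat) : _root_.Int) by rfl, pyGetD_natCast]
/-- xs[i] for 0 ≤ i < len as some-of-the-element. -/
theorem pyGet?_eq_some_getElem (xs : _root_.List α) {i : _root_.Int} (h0 : 0 ≤ i) (h1 : i < xs.length) :
    pyGet? xs i = some (xs[i.toNat]'(by omega)) := by
  rw [pyGet?_of_nonneg xs h0, _root_.List.getElem?_eq_getElem (by omega)]

/-- [f(k) for k in range(a, b)][k] is f(a + k). -/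
theorem pyGetD_map_pyRange_one {β : Type} (f : _root_.Int → β) (a b : _root_.Int) (k : Nat) (d : β) (hk : k < (b - a).toNat) :
    pyGetD ((pyRange a b 1).map f) (k : _root_.Int) d = f (a + k) := by
  simp [_root_.List.getD_eq_getElem?_getD, hk]
/-- [f(k) for k in range(n)][k] is f(k). -/
theorem pyGetD_map_pyRange {β : Type} (f : _root_.Int → β) (n k : Nat) (d : β) (hk : k < n) :
    pyGetD ((pyRange 0 n 1).map f) (k : _root_.Int) d = f k := by
  rw [pyGetD_map_pyRange_one f 0 n k d (by omega)]; simp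
/-- the same at an Int index 0 ≤ i < n (n an Int too — the usual PySem typing). -/
theorem pyGetD_map_pyRange_of_nonneg {β : Type} (f : _root_.Int → β) (n i : _root_.Int) (d : β) (h0 : 0 ≤ i) (h1 : i < n) :
    pyGetD ((pyRange 0 n 1).map f) i d = f i := by
  obtain ⟨k, rfl⟩ := Int.eq_ofNat_of_zero_le h0
  rw [pyGetD_map_pyRange_one f 0 n k d (by omega)]; simp
theorem getElem?_map_pyRange_zero {β : Type} (f : _root_.Int → β) (n k : Nat) (hk : k < n) : ((pyRange 0 n 1).map f)[k]? = some (f k) := by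
  simp [hk]

private theorem filterMap_getElem?_of_map_eq {ι β : Type} (l : _root_.List ι) (g : ι → Nat) (xs ys : _root_.List β)
    (h : l.map (fun k => xs[g k]?) = ys.map some) : l.filterMap (fun k => xs[g k]?) = ys := by
  have e : l.filterMap (fun k => xs[g k]?) = (l.map (fun k => xs[g k]?)).filterMap id := by
    rw [_root_.List.filterMap_map]; rfl
  rw [e, h, _root_.List.filterMap_map]; simp [Function.comp_def]
/-- xs[::-1] is the reversed list. -/
theorem slice?_none_none_neg_one (xs : _root_.List α) : slice? xs none none (-1) = some xs.reverse := by
  unfold slice? sliceIndices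
  have h1 : ¬ ((-1 : _root_.Int) = 0) := by decide
  have h2 : ((-1 : _root_.Int) < 0) := by decide
  have h3 : ¬ ((0 : _root_.Int) < -1) := by decide
  simp only [h1, h2, h3, ↓reduceIte, Option.some.injEq, Int.neg_neg, Int.ediv_one]
  apply filterMap_getElem?_of_map_eq
  apply _root_.List.ext_getElem
  · simp only [_root_.List.length_map, _root_.List.length_range, _root_.List.length_reverse]; split <;> omega
  · intro k hk1 hk2
    simp only [_root_.List.length_map, _root_.List.length_range] at hk1
    have hk : k < xs.length := by simp at hk2; exact hk2
    simp only [_root_.List.getElem_map, _root_.List.getElem_range, _root_.List.getElem_reverse]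
    rw [_root_.List.getElem?_eq_getElem (by omega)]; congr 2; omega
/-- xs[:-1] drops the last element (also on []: both sides []). -/
theorem slice_to_neg_one (xs : _root_.List α) : slice xs none (some (-1)) = xs.dropLast := by
  rw [show (-1 : _root_.Int) = -((1 : Nat) : _root_.Int) by rfl, slice_to_neg_natCast xs 1 (by omega), _root_.List.dropLast_eq_take]
/-- xs[-1:] is the last element as a one-element list ([] on []). -/
theorem slice_from_neg_one (xs : _root_.List α) : slice xs (some (-1)) none = xs.drop (xs.length - 1) := by
  rw [show (-1 : _root_.Int) = -((1 : Nat) : _root_.Int) by rfl, slice_from_neg_natCast xs 1 (by omega)]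
/-- xs[1:] is the tail. -/
theorem slice_from_one (xs : _root_.List α) : slice xs (some 1) none = xs.tail := by
  rw [show (1 : _root_.Int) = ((1 : Nat) : _root_.Int) by rfl, slice_from_natCast, _root_.List.drop_one]

/-- xs.index(v) == k as a split of the list: xs = pre ++ v :: suf with v ∉ pre and len(pre) = k. (Like every index? lemma: rw it BEFORE a plain simp —
@[simp] index?_eq_idxOf? turns index? into core's idxOf? first.) -/
theorem index?_eq_some_iff [BEq α] [LawfulBEq α] (xs : _root_.List α) (v : α) (k : Nat) :
    index? xs v = some k ↔ ∃ pre suf, xs = pre ++ v :: suf ∧ pre.length = k ∧ v ∉ pre := by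
  induction xs generalizing k with
  | nil =>
    simp [index?]
  | cons x t ih =>
    by_cases hx : x = v
    · subst hx
      rw [index?_cons_self]
      constructor
      · intro h; cases h; exact ⟨[], t, rfl, rfl, by simp⟩
      · rintro ⟨pre, suf, he, hl, hn⟩
        cases pre with
        | nil => simpa using hl
        | cons p pre' => exfalso; have : p = x := by simpa using (congrArg _root_.List.head? he).symm
                         exact hn (by simp [this])
    · rw [index?_cons_of_ne t hx]
      constructor
      · intro h
        obtain ⟨k', hk', rfl⟩ := Option.map_eq_some_iff.mp h
        obtain ⟨pre, suf, he, hl, hn⟩ := (ih k').mp hk'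
        exact ⟨x :: pre, suf, by simp [he], by simp [hl], by simp only [_root_.List.mem_cons, not_or]; exact ⟨fun e => hx e.symm, hn⟩⟩
      · rintro ⟨pre, suf, he, hl, hn⟩
        cases pre with
        | nil => exfalso; exact hx (by simpa using (congrArg _root_.List.head? he))
        | cons p pre' =>
          have hp : p = x := by simpa using (congrArg _root_.List.head? he).symm
          subst hp
          have ht : t = pre' ++ v :: suf := by simpa using congrArg _root_.List.tail he
          rw [Option.map_eq_some_iff]
          refine ⟨pre'.length, (ih _).mpr ⟨pre', suf, ht, rfl, fun hm => hn (_root_.List.mem_cons_of_mem _ hm)⟩, ?_⟩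
          simpa using hl
/-- xs.index(v) == k read positionally: v sits at position k and nowhere before it. -/
theorem getElem_of_index?_eq_some [BEq α] [LawfulBEq α] {xs : _root_.List α} {v : α} {k : Nat} (h : index? xs v = some k) :
    ∃ (hk : k < xs.length), xs[k] = v ∧ ∀ (j : Nat) (hj : j < k), xs[j] ≠ v := by
  simp only [index?, _root_.List.idxOf?, _root_.List.findIdx?_eq_some_iff_getElem, beq_iff_eq] at h
  obtain ⟨hk, h1, h2⟩ := h; exact ⟨hk, h1, fun j hj => by simpa using h2 j hj⟩
/-- xs.index(v) for a v in the first part ignores the rest. -/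
theorem index?_append_of_mem [BEq α] [LawfulBEq α] {l : _root_.List α} (t : _root_.List α) {v : α} (h : v ∈ l) : index? (l ++ t) v = index? l v := by
  induction l with
  | nil => simp at h
  | cons x u ih =>
    by_cases hx : x = v
    · subst hx; rw [_root_.List.cons_append, index?_cons_self, index?_cons_self]
    · have hv : v ∈ u := by simpa [Ne.symm hx] using h
      rw [_root_.List.cons_append, index?_cons_of_ne _ hx, index?_cons_of_ne _ hx, ih hv]

private theorem insert_natCast' (l : _root_.List α) (p : Nat) (a : α) : insert l (p : _root_.Int) a = l.take p ++ a :: l.drop p := by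
  simp only [insert, sliceIndices]
  have h1 : ¬ ((1 : _root_.Int) < 0) := by decide
  have h2 : ¬ ((p : _root_.Int) < 0) := by omega
  simp only [h1, h2, ↓reduceIte]
  by_cases hp : p ≤ l.length
  · rw [show min (p : _root_.Int) (l.length : _root_.Int) = p by omega]; simp
  · rw [show min (p : _root_.Int) (l.length : _root_.Int) = l.length by omega]
    have hp' : l.length ≤ p := by omega
    simp [_root_.List.take_of_length_le hp', _root_.List.drop_of_length_le hp']
/-- xs.insert(p, a) at an in-range natural position is take/cons/drop (the bound keeps simp from unfolding an insert it cannot finish; past the end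
Python appends, and so does this form — 'rw [PySem.List.insert_natCast xs p a (by omega)]'). -/
theorem insert_natCast (l : _root_.List α) (p : Nat) (a : α) (_h : p ≤ l.length) : insert l (p : _root_.Int) a = l.take p ++ a :: l.drop p :=
  insert_natCast' l p a
/-- xs.insert(2, v) … with a NUMERAL position. -/
theorem insert_ofNat (l : _root_.List α) (p : Nat) (a : α) (_h : p ≤ l.length) : insert l (no_index (OfNat.ofNat p) : _root_.Int) a = l.take p ++ a :: l.drop p :=
  insert_natCast' l p a
/-- … and the length of that unfolded form (so '(insert xs i v).length' still lands on len + 1 after the unfolding). -/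
@[simp high] theorem length_take_append_cons_drop (l : _root_.List α) (p : Nat) (a : α) : (l.take p ++ a :: l.drop p).length = l.length + 1 := by
  simp; omega
theorem insert_zero (l : _root_.List α) (a : α) : insert l 0 a = a :: l := by
  rw [show (0 : _root_.Int) = ((0 : Nat) : _root_.Int) by rfl, insert_natCast']; simp
theorem insert_length (l : _root_.List α) (a : α) : insert l (l.length : _root_.Int) a = l ++ [a] := by simp [insert_natCast']
theorem insert_len (l : _root_.List α) (a : α) : insert l (len l) a = l ++ [a] := by simp [insert_natCast']

/-- two independent accumulators in one loop are two loops. -/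
theorem foldl_prod_mk {β σ₁ σ₂ : Type} (f : σ₁ → β → σ₁) (g : σ₂ → β → σ₂) (l : _root_.List β) (a : σ₁) (b : σ₂) :
    l.foldl (fun s e => (f s.1 e, g s.2 e)) (a, b) = (l.foldl f a, l.foldl g b) := by
  induction l generalizing a b with
  | nil => rfl
  | cons x t ih => simp [ih]
/-- any() over equal-on-members tests. -/
theorem any_congr_mem {l : _root_.List α} {f g : α → Bool} (h : ∀ x ∈ l, f x = g x) : l.any f = l.any g := by
  induction l with
  | nil => rfl
  | cons x t ih => simp only [_root_.List.any_cons, h x _root_.List.mem_cons_self, ih (fun y hy => h y (_root_.List.mem_cons_of_mem _ hy))]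
/-- a running max bounds every term (Nat / Int). -/
theorem le_foldl_max_nat {β : Type} (xs : _root_.List β) (f : β → Nat) (init : Nat) :
    init ≤ xs.foldl (fun acc y => max acc (f y)) init ∧ ∀ x ∈ xs, f x ≤ xs.foldl (fun acc y => max acc (f y)) init := by
  induction xs generalizing init with
  | nil => simp
  | cons y t ih =>
    simp only [_root_.List.foldl_cons, _root_.List.mem_cons]
    have ⟨h1, h2⟩ := ih (max init (f y))
    exact ⟨by omega, fun x hx => hx.elim (fun e => by subst e; omega) (h2 x)⟩
theorem le_foldl_max_int {β : Type} (xs : _root_.List β) (f : β → _root_.Int) (init : _root_.Int) :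
    init ≤ xs.foldl (fun acc y => max acc (f y)) init ∧ ∀ x ∈ xs, f x ≤ xs.foldl (fun acc y => max acc (f y)) init := by
  induction xs generalizing init with
  | nil => simp
  | cons y t ih =>
    simp only [_root_.List.foldl_cons, _root_.List.mem_cons]
    have ⟨h1, h2⟩ := ih (max init (f y))
    exact ⟨by omega, fun x hx => hx.elim (fun e => by subst e; omega) (h2 x)⟩
/-- xs[i] = v at 0 ≤ i is core's set at i.toNat (both leave the list alone past the end). -/
theorem pySetD_of_nonneg (xs : _root_.List α) {i : _root_.Int} (v : α) (h : 0 ≤ i) : pySetD xs i v = xs.set i.toNat v := by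
  obtain ⟨n, rfl⟩ := Int.eq_ofNat_of_zero_le h; simp
/-- xs[a:b] for any 0 ≤ a, 0 ≤ b (past-the-end bounds clamp exactly as drop/take do). -/
theorem slice_toNat (xs : _root_.List α) {a b : _root_.Int} (ha : 0 ≤ a) (hb : 0 ≤ b) :
    slice xs (some a) (some b) = (xs.drop a.toNat).take (b.toNat - a.toNat) := by
  obtain ⟨m, rfl⟩ := Int.eq_ofNat_of_zero_le ha; obtain ⟨n, rfl⟩ := Int.eq_ofNat_of_zero_le hb
  rw [slice_natCast]; simp

/-! ### Pack 5 — itertools.combinations in CPython's order (index-lexicographic; duplicates in xs are distinct positions). -/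
/-- Python 'list(itertools.combinations(xs, r))' as lists (r a Nat; Python raises on a negative r). -/
def combinations : _root_.List α → Nat → _root_.List (_root_.List α)
  | _, 0 => [[]]
  | [], _ + 1 => []
  | x :: xs, r + 1 => (combinations xs r).map (fun c => x :: c) ++ combinations xs (r + 1)
@[simp] theorem combinations_zero (xs : _root_.List α) : combinations xs 0 = [[]] := by cases xs <;> rfl
@[simp] theorem combinations_nil_succ (r : Nat) : combinations ([] : _root_.List α) (r + 1) = [] := rfl
theorem combinations_cons_succ (x : α) (xs : _root_.List α) (r : Nat) :
    combinations (x :: xs) (r + 1) = (combinations xs r).map (fun c => x :: c) ++ combinations xs (r + 1) := rfl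
/-- the members of combinations(xs, r) are exactly the length-r sublists (order-preserving selections) of xs. -/
theorem mem_combinations_iff : ∀ (xs : _root_.List α) (r : Nat) (c : _root_.List α), c ∈ combinations xs r ↔ c.Sublist xs ∧ c.length = r
  | xs, 0, c => by
    rw [combinations_zero, _root_.List.mem_singleton]
    exact ⟨fun h => h ▸ ⟨_root_.List.nil_sublist _, rfl⟩, fun ⟨_, h⟩ => _root_.List.length_eq_zero_iff.mp h⟩
  | [], r + 1, c => by
    simp only [combinations_nil_succ, _root_.List.not_mem_nil, false_iff, not_and]
    intro hs; rw [_root_.List.sublist_nil.mp hs]; simp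
  | x :: xs, r + 1, c => by
    rw [combinations_cons_succ, _root_.List.mem_append, _root_.List.mem_map, mem_combinations_iff xs (r + 1) c]
    constructor
    · rintro (⟨c', hc', rfl⟩ | ⟨hs, hl⟩)
      · rw [mem_combinations_iff xs r c'] at hc'; exact ⟨hc'.1.cons₂ x, by simp [hc'.2]⟩
      · exact ⟨hs.cons x, hl⟩
    · rintro ⟨hs, hl⟩
      cases hs with
      | cons _ hs' => exact Or.inr ⟨hs', hl⟩
      | cons₂ _ hs' => exact Or.inl ⟨_, (mem_combinations_iff xs r _).mpr ⟨hs', by simpa using hl⟩, rfl⟩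
theorem combinations_eq_nil_of_length_lt (xs : _root_.List α) {r : Nat} (h : xs.length < r) : combinations xs r = [] := by
  apply _root_.List.eq_nil_iff_forall_not_mem.mpr; intro c hc
  obtain ⟨hs, hl⟩ := (mem_combinations_iff xs r c).mp hc
  have := hs.length_le; omega
theorem combinations_one (xs : _root_.List α) : combinations xs 1 = xs.map (fun x => [x]) := by
  induction xs with
  | nil => rfl
  | cons x t ih => rw [combinations_cons_succ, ih, combinations_zero]; rfl
@[simp] theorem combinations_length_self (xs : _root_.List α) : combinations xs xs.length = [xs] := by
  induction xs with
  | nil => rfl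
  | cons x t ih => rw [_root_.List.length_cons, combinations_cons_succ, ih, combinations_eq_nil_of_length_lt t (by omega)]; rfl
theorem length_of_mem_combinations {xs c : _root_.List α} {r : Nat} (h : c ∈ combinations xs r) : c.length = r := ((mem_combinations_iff xs r c).mp h).2
theorem sublist_of_mem_combinations {xs c : _root_.List α} {r : Nat} (h : c ∈ combinations xs r) : c.Sublist xs := ((mem_combinations_iff xs r c).mp h).1
theorem combinations_map {β : Type} (f : α → β) (xs : _root_.List α) (r : Nat) : combinations (xs.map f) r = (combinations xs r).map (_root_.List.map f) := by
  induction xs generalizing r with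
  | nil => cases r <;> rfl
  | cons x t ih => cases r with
    | zero => rfl
    | succ r => simp [combinations_cons_succ, ih, _root_.List.map_append, _root_.List.map_map, Function.comp_def]

/-! ### Lemma pack 6 — 'cite, don't re-derive': indexing a comprehension, xs[i] at 0 ≤ i, 0/1-sums as counts, general-step range,
max with a default, bisect. (Several are one-liners over core lemmas; they exist so a port cites ONE name instead of re-proving it.) -/
section Pack6
variable {β : Type}

/-- 'for x in l: acc.append(x)' — the name ports reach for (= foldl_append_singleton_eq_self). -/
theorem foldl_append_singleton (l acc : _root_.List α) : l.foldl (fun acc x => acc ++ [x]) acc = acc ++ l :=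
  foldl_append_singleton_eq_self l acc
/-- 'n = a; for x in l: if p(x): n += 1' — the name ports reach for (= foldl_if_add_one). -/
theorem foldl_count_if (p : α → Bool) (l : _root_.List α) (a : _root_.Int) :
    l.foldl (fun acc x => if p x then acc + 1 else acc) a = a + (l.countP p : _root_.Int) := foldl_if_add_one p l a

/-- [f(i) for i in range(m)][i] at a Nat index over core's range: f i. -/
theorem getD_map_range (f : Nat → β) (m i : Nat) (d : β) (h : i < m) : ((_root_.List.range m).map f).getD i d = f i := by
  simp [_root_.List.getD_eq_getElem?_getD, h]
/-- [f(x) for x in xs][i] with the matching default: map commutes with getD at EVERY index (no range hypothesis). -/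
theorem getD_map (f : α → β) (xs : _root_.List α) (i : Nat) (d : α) : (xs.map f).getD i (f d) = f (xs.getD i d) := by
  simp only [_root_.List.getD_eq_getElem?_getD, _root_.List.getElem?_map]
  cases xs[i]? <;> rfl
/-- [f(x) for x in xs][i] in range is f xs[i]. -/
theorem getD_map_of_lt (f : α → β) (xs : _root_.List α) (i : Nat) (d : β) (h : i < xs.length) : (xs.map f).getD i d = f xs[i] := by
  simp [_root_.List.getD_eq_getElem?_getD, h]
/-- xs[i] in range at a Nat index is the element (getD form of getElem). -/
theorem getD_eq_getElem_of_lt (xs : _root_.List α) (i : Nat) (d : α) (h : i < xs.length) : xs.getD i d = xs[i] := by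
  simp [_root_.List.getD_eq_getElem?_getD, h]

/-- xs[i] for 0 ≤ i is core's getD at i.toNat (d past the end on both sides). -/
theorem pyGetD_of_nonneg (xs : _root_.List α) {i : _root_.Int} (d : α) (h : 0 ≤ i) : pyGetD xs i d = xs.getD i.toNat d := by
  obtain ⟨n, rfl⟩ := Int.eq_ofNat_of_zero_le h; simp
/-- [f(x) for x in xs][i] = f(xs[i]) at EVERY Int index when the defaults match (negative and out-of-range included). -/
theorem pyGetD_map (f : α → β) (xs : _root_.List α) (i : _root_.Int) (d : α) : pyGetD (xs.map f) i (f d) = f (pyGetD xs i d) := by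
  unfold pyGetD pyGet?
  simp only [_root_.List.length_map]
  cases pyIdx? xs.length i with
  | none => rfl
  | some k => simp only [Option.bind_some, _root_.List.getElem?_map]; cases xs[k]? <;> rfl
/-- [f(x) for x in xs][n] at an in-range natural index. -/
theorem pyGetD_map_natCast (f : α → β) (xs : _root_.List α) (n : Nat) (d : β) (h : n < xs.length) :
    pyGetD (xs.map f) (n : _root_.Int) d = f xs[n] := by
  simp [_root_.List.getD_eq_getElem?_getD, h]
/-- [f(x) for x in xs][i] at an in-range Int index 0 ≤ i < len. -/
theorem pyGetD_map_of_nonneg (f : α → β) (xs : _root_.List α) {i : _root_.Int} (d : β) (h0 : 0 ≤ i) (h1 : i < xs.length) :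
    pyGetD (xs.map f) i d = f (xs[i.toNat]'(by omega)) := by
  obtain ⟨n, rfl⟩ := Int.eq_ofNat_of_zero_le h0
  have hn : n < xs.length := by omega
  simp [_root_.List.getD_eq_getElem?_getD, hn]
/-- xs[2], xs[3], … with a NUMERAL index (the '_natCast' lemmas match a cast '(n : Int)', not a numeral). -/
theorem pyGetD_ofNat' (xs : _root_.List α) (k : Nat) (d : α) : pyGetD xs (no_index (OfNat.ofNat k) : _root_.Int) d = xs.getD k d :=
  pyGetD_natCast xs k d
theorem pyGet?_ofNat' (xs : _root_.List α) (k : Nat) : pyGet? xs (no_index (OfNat.ofNat k) : _root_.Int) = xs[k]? :=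
  pyGet?_natCast xs k

/-- 'for i in range(len(xs)): … f(xs[i]) …' as a comprehension is the comprehension over the elements. Cite with f given explicitly —
'rw [map_pyRange_zero_pyGetD xs d (fun v => v + 1)]' — simp will not find it for a compound body. -/
theorem map_pyRange_zero_pyGetD (xs : _root_.List α) (d : α) (f : α → β) :
    (pyRange 0 (len xs) 1).map (fun j => f (pyGetD xs j d)) = xs.map f := by
  rw [show (fun j => f (pyGetD xs j d)) = f ∘ (fun j => pyGetD xs j d) from rfl, ← _root_.List.map_map, map_pyGetD_pyRange_zero]
theorem map_pyRange_zero_pyGetD' (xs : _root_.List α) (d : α) (f : α → β) :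
    (pyRange 0 (xs.length : _root_.Int) 1).map (fun j => f (pyGetD xs j d)) = xs.map f := map_pyRange_zero_pyGetD xs d f

/-- sum(1 for x in xs if p(x)) / sum(p(x) for x in xs): a 0/1-sum is a count (Int, Bool test). -/
theorem sum_map_ite_one_zero (p : α → Bool) (xs : _root_.List α) :
    (xs.map (fun x => if p x then (1 : _root_.Int) else 0)).sum = (xs.countP p : _root_.Int) := by
  induction xs with
  | nil => simp
  | cons x t ih => cases hp : p x <;> simp [hp, ih] <;> omega
/-- the same with a Prop test. -/
theorem sum_map_ite_one_zero' (p : α → Prop) [DecidablePred p] (xs : _root_.List α) :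
    (xs.map (fun x => if p x then (1 : _root_.Int) else 0)).sum = (xs.countP (fun x => decide (p x)) : _root_.Int) := by
  induction xs with
  | nil => simp
  | cons x t ih => by_cases hp : p x <;> simp [hp, ih] <;> omega
/-- Nat-valued 0/1-sums. -/
theorem sum_map_ite_one_zero_nat (p : α → Bool) (xs : _root_.List α) :
    (xs.map (fun x => if p x then (1 : Nat) else 0)).sum = xs.countP p := by
  induction xs with
  | nil => simp
  | cons x t ih => cases hp : p x <;> simp [hp, ih] <;> omega
theorem sum_map_ite_one_zero_nat' (p : α → Prop) [DecidablePred p] (xs : _root_.List α) :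
    (xs.map (fun x => if p x then (1 : Nat) else 0)).sum = xs.countP (fun x => decide (p x)) := by
  induction xs with
  | nil => simp
  | cons x t ih => by_cases hp : p x <;> simp [hp, ih] <;> omega
/-- sum(int(b) for b in bools) with Bool.toNat. -/
theorem sum_map_toNat (p : α → Bool) (xs : _root_.List α) : (xs.map (fun x => (p x).toNat)).sum = xs.countP p := by
  induction xs with
  | nil => simp
  | cons x t ih => cases hp : p x <;> simp [hp, ih] <;> omega
/-- sum(c for _ in xs) is len(xs) * c. -/
theorem sum_map_const_int (xs : _root_.List α) (c : _root_.Int) : (xs.map (fun _ => c)).sum = (xs.length : _root_.Int) * c := by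
  induction xs with
  | nil => simp
  | cons x t ih => simp [ih, Int.add_mul, Int.add_comm]
theorem sum_map_const_nat (xs : _root_.List α) (c : Nat) : (xs.map (fun _ => c)).sum = xs.length * c := by
  induction xs with
  | nil => simp
  | cons x t ih => simp [ih, Nat.add_mul, Nat.add_comm]
/-- sum over an appended element (the loop step of 'total += x' read back as a sum). -/
theorem sum_append_singleton_int (xs : _root_.List _root_.Int) (x : _root_.Int) : (xs ++ [x]).sum = xs.sum + x := by
  simp
/-- sum(f(x) + g(x) for x in xs) splits. -/
theorem sum_map_add_int (xs : _root_.List α) (f g : α → _root_.Int) :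
    (xs.map (fun x => f x + g x)).sum = (xs.map f).sum + (xs.map g).sum := by
  induction xs with
  | nil => simp
  | cons x t ih => simp [ih]; omega
/-- sum(c * f(x) for x in xs) = c * sum(...). -/
theorem sum_map_const_mul_int (xs : _root_.List α) (c : _root_.Int) (f : α → _root_.Int) :
    (xs.map (fun x => c * f x)).sum = c * (xs.map f).sum := by
  induction xs with
  | nil => simp
  | cons x t ih => simp [ih, Int.mul_add]

/-- range(n) with n a natural, under the name ports reach for (= pyRange_zero_nat). -/
theorem pyRange_zero_natCast (n : Nat) : pyRange 0 (n : _root_.Int) 1 = (_root_.List.range n).map fun (k : Nat) => (k : _root_.Int) :=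
  pyRange_zero_nat n
/-- range(a, b, s) for a POSITIVE step as an explicit map over core's range: a, a+s, a+2s, … (count = ceil((b-a)/s), 0 if b ≤ a). -/
theorem pyRange_of_pos (a b : _root_.Int) {s : _root_.Int} (hs : 0 < s) :
    pyRange a b s = (_root_.List.range (if a < b then ((b - a + s - 1) / s).toNat else 0)).map fun (k : Nat) => a + s * (k : _root_.Int) := by
  unfold pyRange
  have h1 : s ≠ 0 := by omega
  simp [h1, hs]
/-- range(a, b, s) for a NEGATIVE step: a, a+s, … counting down (count = ceil((a-b)/(-s)), 0 if a ≤ b). -/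
theorem pyRange_of_neg (a b : _root_.Int) {s : _root_.Int} (hs : s < 0) :
    pyRange a b s = (_root_.List.range (if b < a then ((a - b + (-s) - 1) / (-s)).toNat else 0)).map fun (k : Nat) => a + s * (k : _root_.Int) := by
  unfold pyRange
  have h1 : s ≠ 0 := by omega
  have h2 : ¬ 0 < s := by omega
  simp [h1, h2]
/-- every element of range(a, b, s), s > 0, lies in [a, b) and is a + s*k. -/
theorem mem_pyRange_of_pos {a b s x : _root_.Int} (hs : 0 < s) (hx : x ∈ pyRange a b s) : a ≤ x ∧ x < b ∧ ∃ k : Nat, x = a + s * k := by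
  rw [pyRange_of_pos a b hs, _root_.List.mem_map] at hx
  obtain ⟨k, hk, rfl⟩ := hx
  rw [_root_.List.mem_range] at hk
  split at hk
  · rename_i hab
    refine ⟨by have := Int.mul_nonneg (Int.le_of_lt hs) (Int.natCast_nonneg k); omega, ?_, k, rfl⟩
    have hk' : (k : _root_.Int) + 1 ≤ (b - a + s - 1) / s := by omega
    have := (Int.le_ediv_iff_mul_le hs).mp hk'
    have e : ((k : _root_.Int) + 1) * s = s * k + s := by rw [Int.add_mul, Int.one_mul, Int.mul_comm]
    omega
  · omega
/-- every element of range(a, b, s), s < 0, lies in (b, a]. -/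
theorem mem_pyRange_of_neg {a b s x : _root_.Int} (hs : s < 0) (hx : x ∈ pyRange a b s) : b < x ∧ x ≤ a ∧ ∃ k : Nat, x = a + s * k := by
  rw [pyRange_of_neg a b hs, _root_.List.mem_map] at hx
  obtain ⟨k, hk, rfl⟩ := hx
  rw [_root_.List.mem_range] at hk
  split at hk
  · rename_i hab
    have hs' : 0 < -s := by omega
    refine ⟨?_, by have := Int.mul_nonneg (Int.le_of_lt hs') (Int.natCast_nonneg k); rw [Int.neg_mul] at this; omega, k, rfl⟩
    have hk' : (k : _root_.Int) + 1 ≤ (a - b + (-s) - 1) / (-s) := by omega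
    have := (Int.le_ediv_iff_mul_le hs').mp hk'
    have e : ((k : _root_.Int) + 1) * (-s) = -(s * k) - s := by rw [Int.add_mul, Int.one_mul, Int.mul_comm, Int.neg_mul]; omega
    omega
  · omega

theorem length_pyRange_of_pos (a b : _root_.Int) {s : _root_.Int} (hs : 0 < s) :
    (pyRange a b s).length = if a < b then ((b - a + s - 1) / s).toNat else 0 := by
  simp [pyRange_of_pos a b hs]
theorem length_pyRange_of_neg (a b : _root_.Int) {s : _root_.Int} (hs : s < 0) :
    (pyRange a b s).length = if b < a then ((a - b + (-s) - 1) / (-s)).toNat else 0 := by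
  simp [pyRange_of_neg a b hs]
/-- membership in range(a, b, s), s > 0: in [a, b) and on the stride. -/
theorem mem_pyRange_iff_of_pos {a b s : _root_.Int} (hs : 0 < s) (x : _root_.Int) : x ∈ pyRange a b s ↔ a ≤ x ∧ x < b ∧ s ∣ (x - a) := by
  constructor
  · intro hx
    obtain ⟨h1, h2, k, hk⟩ := mem_pyRange_of_pos hs hx
    exact ⟨h1, h2, ⟨k, by omega⟩⟩
  · rintro ⟨h1, h2, ⟨c, hc⟩⟩
    rw [pyRange_of_pos a b hs, _root_.List.mem_map]
    have hc0 : 0 ≤ c := Int.le_of_mul_le_mul_left (a := s) (by omega) hs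
    refine ⟨c.toNat, ?_, by rw [Int.toNat_of_nonneg hc0]; omega⟩
    rw [_root_.List.mem_range]
    have hab : a < b := by omega
    simp only [hab, ↓reduceIte]
    have : c + 1 ≤ (b - a + s - 1) / s := (Int.le_ediv_iff_mul_le hs).mpr (by rw [Int.add_mul, Int.one_mul, Int.mul_comm]; omega)
    omega
/-- membership in range(a, b, s), s < 0: in (b, a] and on the stride. -/
theorem mem_pyRange_iff_of_neg {a b s : _root_.Int} (hs : s < 0) (x : _root_.Int) : x ∈ pyRange a b s ↔ b < x ∧ x ≤ a ∧ s ∣ (x - a) := by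
  constructor
  · intro hx
    obtain ⟨h1, h2, k, hk⟩ := mem_pyRange_of_neg hs hx
    exact ⟨h1, h2, ⟨k, by omega⟩⟩
  · rintro ⟨h1, h2, ⟨c, hc⟩⟩
    rw [pyRange_of_neg a b hs, _root_.List.mem_map]
    have hs' : 0 < -s := by omega
    have hc0 : 0 ≤ c := Int.le_of_mul_le_mul_left (a := -s) (by rw [Int.neg_mul, Int.neg_mul]; omega) hs'
    refine ⟨c.toNat, ?_, by rw [Int.toNat_of_nonneg hc0]; omega⟩
    rw [_root_.List.mem_range]
    have hab : b < a := by omega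
    simp only [hab, ↓reduceIte]
    have : c + 1 ≤ (a - b + (-s) - 1) / (-s) := (Int.le_ediv_iff_mul_le hs').mpr (by rw [Int.add_mul, Int.one_mul, Int.mul_comm, Int.neg_mul]; omega)
    omega

/-- Python max(xs, key=key, default=d) / max of a list known non-empty: the FIRST maximal element, d on []. -/
def maxD {κ : Type} [LT κ] [DecidableLT κ] (xs : _root_.List α) (key : α → κ) (d : α) : α := (max? xs key).getD d
/-- Python min(xs, key=key, default=d). -/
def minD {κ : Type} [LT κ] [DecidableLT κ] (xs : _root_.List α) (key : α → κ) (d : α) : α := (min? xs key).getD d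
@[simp] theorem maxD_nil {κ : Type} [LT κ] [DecidableLT κ] (key : α → κ) (d : α) : maxD [] key d = d := rfl
@[simp] theorem minD_nil {κ : Type} [LT κ] [DecidableLT κ] (key : α → κ) (d : α) : minD [] key d = d := rfl
theorem max?_eq_some_maxD {κ : Type} [LT κ] [DecidableLT κ] (xs : _root_.List α) (key : α → κ) (d : α) (h : xs ≠ []) :
    max? xs key = some (maxD xs key d) := by
  unfold maxD
  cases hm : max? xs key with
  | none => exact absurd ((max?_eq_none_iff xs key).mp hm) h
  | some m => rfl
theorem min?_eq_some_minD {κ : Type} [LT κ] [DecidableLT κ] (xs : _root_.List α) (key : α → κ) (d : α) (h : xs ≠ []) :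
    min? xs key = some (minD xs key d) := by
  unfold minD
  cases hm : min? xs key with
  | none => exact absurd ((min?_eq_none_iff xs key).mp hm) h
  | some m => rfl
theorem maxD_mem {κ : Type} [LT κ] [DecidableLT κ] (xs : _root_.List α) (key : α → κ) (d : α) (h : xs ≠ []) : maxD xs key d ∈ xs :=
  max?_mem (max?_eq_some_maxD xs key d h)
theorem minD_mem {κ : Type} [LT κ] [DecidableLT κ] (xs : _root_.List α) (key : α → κ) (d : α) (h : xs ≠ []) : minD xs key d ∈ xs :=
  min?_mem (min?_eq_some_minD xs key d h)

/-- Python 'list(itertools.permutations(xs, r))' as lists, in CPython's order (index-lexicographic; equal elements at different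
positions count as distinct). 'itertools.permutations(xs)' is 'permutations xs xs.length'. r > len gives []. -/
def permutations : _root_.List α → Nat → _root_.List (_root_.List α)
  | _, 0 => [[]]
  | xs, r + 1 => (_root_.List.range xs.length).flatMap fun i =>
      match xs[i]? with
      | none => []
      | some x => (permutations (xs.eraseIdx i) r).map (fun p => x :: p)

@[simp] theorem permutations_zero (xs : _root_.List α) : permutations xs 0 = [[]] := by cases xs <;> rfl
@[simp] theorem permutations_nil_succ (r : Nat) : permutations ([] : _root_.List α) (r + 1) = [] := rfl
theorem permutations_succ (xs : _root_.List α) (r : Nat) :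
    permutations xs (r + 1) = (_root_.List.range xs.length).flatMap (fun i =>
      match xs[i]? with
      | none => []
      | some x => (permutations (xs.eraseIdx i) r).map (fun p => x :: p)) := by
  cases xs <;> rfl

/-- the element at position i, consed onto the list without it, is a permutation of the list. -/
theorem perm_cons_eraseIdx (xs : _root_.List α) {i : Nat} {x : α} (h : xs[i]? = some x) : (x :: xs.eraseIdx i).Perm xs := by
  have hi : i < xs.length := (_root_.List.getElem?_eq_some_iff.mp h).1
  have hx : xs[i] = x := (_root_.List.getElem?_eq_some_iff.mp h).2
  rw [_root_.List.eraseIdx_eq_take_drop_succ]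
  have e : xs = xs.take i ++ x :: xs.drop (i + 1) := by
    conv => lhs; rw [← _root_.List.take_append_drop i xs]
    rw [← hx, _root_.List.getElem_cons_drop]
  conv => rhs; rw [e]
  exact _root_.List.perm_middle.symm

/-- every member of permutations(xs, r) has length r and extends to a permutation of xs. -/
theorem exists_perm_of_mem_permutations : ∀ (r : Nat) (xs p : _root_.List α), p ∈ permutations xs r →
    p.length = r ∧ ∃ rest : _root_.List α, (p ++ rest).Perm xs
  | 0, xs, p, h => by
    rw [permutations_zero, _root_.List.mem_singleton] at h; subst h; exact ⟨rfl, xs, _root_.List.Perm.refl _⟩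
  | r + 1, xs, p, h => by
    rw [permutations_succ, _root_.List.mem_flatMap] at h
    obtain ⟨i, hi, hp⟩ := h
    rw [_root_.List.mem_range] at hi
    have hsome : xs[i]? = some xs[i] := _root_.List.getElem?_eq_getElem hi
    simp only [hsome, _root_.List.mem_map] at hp
    obtain ⟨q, hq, rfl⟩ := hp
    obtain ⟨hlen, rest, hrest⟩ := exists_perm_of_mem_permutations r (xs.eraseIdx i) q hq
    refine ⟨by simp [hlen], rest, ?_⟩
    rw [_root_.List.cons_append]
    exact ((hrest.cons xs[i]).trans (perm_cons_eraseIdx xs hsome))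

theorem length_of_mem_permutations {xs p : _root_.List α} {r : Nat} (h : p ∈ permutations xs r) : p.length = r :=
  (exists_perm_of_mem_permutations r xs p h).1
/-- a member of permutations(xs) (r = len) IS a permutation of xs. -/
theorem perm_of_mem_permutations {xs p : _root_.List α} (h : p ∈ permutations xs xs.length) : p.Perm xs := by
  obtain ⟨hlen, rest, hrest⟩ := exists_perm_of_mem_permutations xs.length xs p h
  have h1 := hrest.length_eq
  rw [_root_.List.length_append, hlen] at h1
  have : rest = [] := _root_.List.length_eq_zero_iff.mp (by omega)
  subst this; simpa using hrest
/-- members of permutations(xs, r) draw their elements from xs. -/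
theorem mem_of_mem_of_mem_permutations {xs p : _root_.List α} {r : Nat} {y : α} (h : p ∈ permutations xs r) (hy : y ∈ p) : y ∈ xs := by
  obtain ⟨_, rest, hrest⟩ := exists_perm_of_mem_permutations r xs p h
  exact hrest.mem_iff.mp (_root_.List.mem_append_left rest hy)
theorem permutations_eq_nil_of_length_lt : ∀ (r : Nat) (xs : _root_.List α), xs.length < r → permutations xs r = []
  | 0, xs, h => absurd h (Nat.not_lt_zero _)
  | r + 1, xs, h => by
    apply _root_.List.eq_nil_iff_forall_not_mem.mpr; intro p hp
    obtain ⟨hlen, rest, hrest⟩ := exists_perm_of_mem_permutations (r + 1) xs p hp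
    have := hrest.length_eq; simp at this; omega

/-- Python bisect.bisect_left(xs, x): CPython's loop exactly (lo = 0, hi = len; while lo < hi: mid = (lo+hi)//2; if xs[mid] < x: lo = mid+1
else: hi = mid), on a fuel of len steps (the loop takes at most that many). Exact on EVERY list; meaningful (the sorted-insertion point) on sorted ones. -/
def bisectLeftLoop [LT α] [DecidableLT α] (xs : _root_.List α) (x : α) : Nat → Nat → Nat → Nat
  | 0, lo, _ => lo
  | fuel + 1, lo, hi =>
    if lo < hi then
      match xs[(lo + hi) / 2]? with
      | some y => if y < x then bisectLeftLoop xs x fuel ((lo + hi) / 2 + 1) hi else bisectLeftLoop xs x fuel lo ((lo + hi) / 2)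
      | none => lo
    else lo
def bisectLeft [LT α] [DecidableLT α] (xs : _root_.List α) (x : α) : Nat := bisectLeftLoop xs x xs.length 0 xs.length
/-- Python bisect.bisect_right(xs, x) (= bisect.bisect): as bisect_left with the test 'x < xs[mid]' choosing the left half. -/
def bisectRightLoop [LT α] [DecidableLT α] (xs : _root_.List α) (x : α) : Nat → Nat → Nat → Nat
  | 0, lo, _ => lo
  | fuel + 1, lo, hi =>
    if lo < hi then
      match xs[(lo + hi) / 2]? with
      | some y => if x < y then bisectRightLoop xs x fuel lo ((lo + hi) / 2) else bisectRightLoop xs x fuel ((lo + hi) / 2 + 1) hi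
      | none => lo
    else lo
def bisectRight [LT α] [DecidableLT α] (xs : _root_.List α) (x : α) : Nat := bisectRightLoop xs x xs.length 0 xs.length
@[simp] theorem bisectLeft_nil [LT α] [DecidableLT α] (x : α) : bisectLeft ([] : _root_.List α) x = 0 := rfl
@[simp] theorem bisectRight_nil [LT α] [DecidableLT α] (x : α) : bisectRight ([] : _root_.List α) x = 0 := rfl
/-- the loop invariant of bisect_left on a SORTED Int list: everything left of the result is < x, everything from it on is ≥ x. -/
theorem bisectLeftLoop_spec (xs : _root_.List _root_.Int) (x : _root_.Int) (hs : xs.Pairwise (· ≤ ·)) :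
    ∀ (fuel lo hi : Nat), lo ≤ hi → hi ≤ xs.length → hi - lo ≤ fuel →
      (∀ (j : Nat) (hj : j < xs.length), j < lo → xs[j] < x) → (∀ (j : Nat) (hj : j < xs.length), hi ≤ j → x ≤ xs[j]) →
      lo ≤ bisectLeftLoop xs x fuel lo hi ∧ bisectLeftLoop xs x fuel lo hi ≤ hi ∧
      (∀ (j : Nat) (hj : j < xs.length), j < bisectLeftLoop xs x fuel lo hi → xs[j] < x) ∧
      (∀ (j : Nat) (hj : j < xs.length), bisectLeftLoop xs x fuel lo hi ≤ j → x ≤ xs[j]) := by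
  have hmono : ∀ (i j : Nat) (hi : i < xs.length) (hj : j < xs.length), i ≤ j → xs[i] ≤ xs[j] := by
    intro i j hi hj hij
    rcases Nat.lt_or_eq_of_le hij with h | h
    · exact _root_.List.pairwise_iff_getElem.mp hs i j hi hj h
    · subst h; exact Int.le_refl _
  intro fuel
  induction fuel with
  | zero =>
    intro lo hi h1 h2 h3 hL hR
    have e : lo = hi := by omega
    subst e
    simp only [bisectLeftLoop]
    exact ⟨Nat.le_refl _, Nat.le_refl _, fun j hj h => hL j hj h, fun j hj h => hR j hj h⟩
  | succ fuel ih =>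
    intro lo hi h1 h2 h3 hL hR
    simp only [bisectLeftLoop]
    by_cases hlt : lo < hi
    · simp only [hlt, ↓reduceIte]
      have hmid : (lo + hi) / 2 < xs.length := by omega
      rw [_root_.List.getElem?_eq_getElem hmid]
      simp only
      by_cases hy : xs[(lo + hi) / 2] < x
      · simp only [hy, ↓reduceIte]
        have := ih ((lo + hi) / 2 + 1) hi (by omega) h2 (by omega)
          (fun j hj hjl => by have := hmono j ((lo + hi) / 2) hj hmid (by omega); omega) hR
        exact ⟨by omega, this.2.1, this.2.2.1, this.2.2.2⟩
      · simp only [hy, ↓reduceIte]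
        have := ih lo ((lo + hi) / 2) (by omega) (by omega) (by omega) hL
          (fun j hj hjm => by have := hmono ((lo + hi) / 2) j hmid hj hjm; omega)
        exact ⟨this.1, by omega, this.2.2.1, this.2.2.2⟩
    · simp only [hlt, ↓reduceIte]
      have e : lo = hi := by omega
      subst e
      exact ⟨Nat.le_refl _, Nat.le_refl _, fun j hj h => hL j hj h, fun j hj h => hR j hj h⟩

/-- bisect_left on a sorted Int list: the insertion point — all of xs[:r] < x ≤ all of xs[r:], r ≤ len. -/
theorem bisectLeft_spec (xs : _root_.List _root_.Int) (x : _root_.Int) (hs : xs.Pairwise (· ≤ ·)) :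
    bisectLeft xs x ≤ xs.length ∧ (∀ (j : Nat) (hj : j < xs.length), j < bisectLeft xs x → xs[j] < x) ∧
      (∀ (j : Nat) (hj : j < xs.length), bisectLeft xs x ≤ j → x ≤ xs[j]) := by
  have h := bisectLeftLoop_spec xs x hs xs.length 0 xs.length (by omega) (by omega) (by omega) (fun _ _ h => absurd h (Nat.not_lt_zero _)) (fun j hj h => by omega)
  exact ⟨h.2.1, h.2.2.1, h.2.2.2⟩

theorem bisectRightLoop_spec (xs : _root_.List _root_.Int) (x : _root_.Int) (hs : xs.Pairwise (· ≤ ·)) :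
    ∀ (fuel lo hi : Nat), lo ≤ hi → hi ≤ xs.length → hi - lo ≤ fuel →
      (∀ (j : Nat) (hj : j < xs.length), j < lo → xs[j] ≤ x) → (∀ (j : Nat) (hj : j < xs.length), hi ≤ j → x < xs[j]) →
      lo ≤ bisectRightLoop xs x fuel lo hi ∧ bisectRightLoop xs x fuel lo hi ≤ hi ∧
      (∀ (j : Nat) (hj : j < xs.length), j < bisectRightLoop xs x fuel lo hi → xs[j] ≤ x) ∧
      (∀ (j : Nat) (hj : j < xs.length), bisectRightLoop xs x fuel lo hi ≤ j → x < xs[j]) := by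
  have hmono : ∀ (i j : Nat) (hi : i < xs.length) (hj : j < xs.length), i ≤ j → xs[i] ≤ xs[j] := by
    intro i j hi hj hij
    rcases Nat.lt_or_eq_of_le hij with h | h
    · exact _root_.List.pairwise_iff_getElem.mp hs i j hi hj h
    · subst h; exact Int.le_refl _
  intro fuel
  induction fuel with
  | zero =>
    intro lo hi h1 h2 h3 hL hR
    have e : lo = hi := by omega
    subst e
    simp only [bisectRightLoop]
    exact ⟨Nat.le_refl _, Nat.le_refl _, fun j hj h => hL j hj h, fun j hj h => hR j hj h⟩
  | succ fuel ih =>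
    intro lo hi h1 h2 h3 hL hR
    simp only [bisectRightLoop]
    by_cases hlt : lo < hi
    · simp only [hlt, ↓reduceIte]
      have hmid : (lo + hi) / 2 < xs.length := by omega
      rw [_root_.List.getElem?_eq_getElem hmid]
      simp only
      by_cases hy : x < xs[(lo + hi) / 2]
      · simp only [hy, ↓reduceIte]
        have := ih lo ((lo + hi) / 2) (by omega) (by omega) (by omega) hL
          (fun j hj hjm => by have := hmono ((lo + hi) / 2) j hmid hj hjm; omega)
        exact ⟨this.1, by omega, this.2.2.1, this.2.2.2⟩
      · simp only [hy, ↓reduceIte]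
        have := ih ((lo + hi) / 2 + 1) hi (by omega) h2 (by omega)
          (fun j hj hjl => by have := hmono j ((lo + hi) / 2) hj hmid (by omega); omega) hR
        exact ⟨by omega, this.2.1, this.2.2.1, this.2.2.2⟩
    · simp only [hlt, ↓reduceIte]
      have e : lo = hi := by omega
      subst e
      exact ⟨Nat.le_refl _, Nat.le_refl _, fun j hj h => hL j hj h, fun j hj h => hR j hj h⟩

/-- bisect_right on a sorted Int list: all of xs[:r] ≤ x < all of xs[r:], r ≤ len. -/
theorem bisectRight_spec (xs : _root_.List _root_.Int) (x : _root_.Int) (hs : xs.Pairwise (· ≤ ·)) :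
    bisectRight xs x ≤ xs.length ∧ (∀ (j : Nat) (hj : j < xs.length), j < bisectRight xs x → xs[j] ≤ x) ∧
      (∀ (j : Nat) (hj : j < xs.length), bisectRight xs x ≤ j → x < xs[j]) := by
  have h := bisectRightLoop_spec xs x hs xs.length 0 xs.length (by omega) (by omega) (by omega) (fun _ _ h => absurd h (Nat.not_lt_zero _)) (fun j hj h => by omega)
  exact ⟨h.2.1, h.2.2.1, h.2.2.2⟩

end Pack6

end List

/-! ## Set — Python 'set' as the list of its elements in FIRST-INSERTION order, without duplicates (lemma pack 3).
EXACT AS SETS: membership, add, discard/remove?, len, | (union) & (inter) - (diff) ^ (symmDiff), issubset/issuperset/isdisjoint,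
== (Set.equal — NOT '=' / '==', which compare the underlying lists order-sensitively) and set(xs) (Set.ofList). A Set value must be
BUILT by empty/ofList/add/update/union/inter/diff/symmDiff/discard: a plain list with duplicates is not set(xs) — write Set.ofList xs.
NOT MODELLED: Python's ITERATION order over a set (hash order). The order here (first insertion) is a model choice, so a port may consume
a Set's elements only where the result cannot depend on their order: sum / any / all, min / max / sorted WITHOUT a key (or with a key that
is injective on the set), membership tests, building another Set, or a Dict that is afterwards only looked up. NOT exact — do not port
through a Set's order: list(s), [f(x) for x in s], 'for x in s: out.append(…)' / '"".join(s)' / break-on-first-hit, s.pop(), next(iter(s)),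
enumerate(s), zip(s, …), returning a dict built by iterating s, sorted(s, key=k) with ties under k. If the Python's RESULT depends on set
order, the Python itself is hash-order dependent: say so (NOT_PORTABLE) rather than silently using this order.
The type is 'List α' itself (an abbreviation): a Set is returned where a signature says List T, '∈' and the List lemmas apply, 'decide'
evaluates it. On a value TYPED 'List T' dot-notation finds core/Mathlib List functions, not these (xs.insert PREPENDS, xs.union /
xs.dedup differ) — write 'PySem.Set.add s x', 'PySem.Set.ofList xs', or type the value 'PySem.Set T'. -/
abbrev Set (α : Type) := _root_.List α

namespace Set

variable {α : Type} [BEq α]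

/-- 'set()'. -/
def empty : Set α := []
/-- 'x in s'. -/
def contains (s : Set α) (x : α) : Bool := _root_.List.contains s x
/-- 's.add(x)': no-op if present, else x becomes the newest element. -/
def add (s : Set α) (x : α) : Set α := if s.contains x then s else s ++ [x]
/-- 'set(xs)' / '{… for x in xs}' / also 'list(dict.fromkeys(xs))': first occurrences, in order. -/
def ofList (xs : _root_.List α) : Set α := xs.foldl add empty
/-- 's.update(xs)' / 's |= set(xs)'. -/
def update (s : Set α) (xs : _root_.List α) : Set α := xs.foldl add s
/-- 's | t'. -/
def union (s t : Set α) : Set α := update s t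
/-- 's & t' (elements of s that are in t, in s's order). -/
def inter (s t : Set α) : Set α := s.filter (fun x => t.contains x)
/-- 's - t'. -/
def diff (s t : Set α) : Set α := s.filter (fun x => !t.contains x)
/-- 's.discard(x)' (absent x: unchanged). -/
def discard (s : Set α) (x : α) : Set α := s.filter (fun y => !(y == x))
/-- 's.remove(x)': none = KeyError when x is absent. -/
def remove? (s : Set α) (x : α) : Option (Set α) := if s.contains x then some (discard s x) else none
/-- 's <= t' / 's.issubset(t)'. -/
def issubset (s t : Set α) : Bool := s.all (fun x => t.contains x)
/-- 's ^ t' (symmetric difference: s's survivors, then t's). -/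
def symmDiff (s t : Set α) : Set α := diff s t ++ diff t s
/-- 's >= t' / 's.issuperset(t)'. -/
def issuperset (s t : Set α) : Bool := issubset t s
/-- 's == t' as SETS (same members). '=' / '==' on Set compare the element LISTS and are order-sensitive — not Python's ==. -/
def equal (s t : Set α) : Bool := issubset s t && issubset t s
/-- 's.isdisjoint(t)'. -/
def isdisjoint (s t : Set α) : Bool := !s.any (fun x => t.contains x)
/-- 'len(s)' as an Int. -/
def len (s : Set α) : _root_.Int := s.length

omit [BEq α] in @[simp] theorem empty_eq : (empty : Set α) = [] := rfl
omit [BEq α] in @[simp] theorem len_eq (s : Set α) : len s = s.length := rfl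
theorem ofList_eq_foldl (xs : _root_.List α) : ofList xs = xs.foldl add [] := rfl
@[simp] theorem ofList_nil : ofList ([] : _root_.List α) = [] := rfl
theorem update_eq_foldl (s : Set α) (xs : _root_.List α) : update s xs = xs.foldl add s := rfl
theorem union_eq_update (s t : Set α) : union s t = update s t := rfl
@[simp] theorem update_nil (s : Set α) : update s [] = s := rfl
@[simp] theorem update_cons (s : Set α) (x : α) (xs : _root_.List α) : update s (x :: xs) = update (add s x) xs := rfl
theorem update_append (s : Set α) (xs ys : _root_.List α) : update s (xs ++ ys) = update (update s xs) ys := by simp [update]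
/-- set(xs) one element at a time from the RIGHT (the induction-friendly form for 'xs ++ [x]'). -/
theorem ofList_append_singleton (xs : _root_.List α) (x : α) : ofList (xs ++ [x]) = add (ofList xs) x := by simp [ofList, add]
theorem ofList_append (xs ys : _root_.List α) : ofList (xs ++ ys) = update (ofList xs) ys := by simp [ofList, update]

section Lawful
variable [LawfulBEq α]

omit [LawfulBEq α] in @[simp] theorem contains_eq_listContains (s : Set α) (x : α) : contains s x = _root_.List.contains s x := rfl
theorem contains_iff (s : Set α) (x : α) : contains s x = true ↔ x ∈ s := by simp
theorem contains_eq_decide [DecidableEq α] (s : Set α) (x : α) : contains s x = decide (x ∈ s) := by simp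
/-- s.add(x) spelled with '∈' (how a hand port writes it). -/
theorem add_eq_ite (s : Set α) (x : α) : add s x = if x ∈ s then s else s ++ [x] := by simp [add]
@[simp] theorem add_of_mem {s : Set α} {x : α} (h : x ∈ s) : add s x = s := by simp [add, h]
@[simp] theorem add_of_not_mem {s : Set α} {x : α} (h : x ∉ s) : add s x = s ++ [x] := by simp [add, h]
@[simp] theorem mem_add (s : Set α) (x y : α) : y ∈ add s x ↔ y ∈ s ∨ y = x := by
  by_cases h : x ∈ s
  · simp [h]; intro e; exact e ▸ h
  · simp [h]
theorem nodup_add (s : Set α) (x : α) (h : s.Nodup) : (add s x).Nodup := by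
  by_cases hx : x ∈ s
  · simpa [hx]
  · rw [add_of_not_mem hx, _root_.List.nodup_append]
    refine ⟨h, by simp, ?_⟩
    intro a ha b hb; simp at hb; subst hb; intro hab; subst hab; exact hx ha
@[simp] theorem mem_update (s : Set α) (xs : _root_.List α) (y : α) : y ∈ update s xs ↔ y ∈ s ∨ y ∈ xs := by
  induction xs generalizing s with
  | nil => simp
  | cons x t ih => simp [ih, or_assoc]
theorem nodup_update (s : Set α) (xs : _root_.List α) (h : s.Nodup) : (update s xs).Nodup := by
  induction xs generalizing s with
  | nil => simpa
  | cons x t ih => exact ih _ (nodup_add s x h)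
/-- set(xs) has exactly the members of xs, once each. -/
@[simp] theorem mem_ofList (xs : _root_.List α) (y : α) : y ∈ ofList xs ↔ y ∈ xs := by simp [ofList, ← update_eq_foldl]
@[simp] theorem nodup_ofList (xs : _root_.List α) : (ofList xs).Nodup := by rw [ofList, ← update_eq_foldl]; exact nodup_update _ _ _root_.List.nodup_nil
@[simp] theorem mem_union (s t : Set α) (y : α) : y ∈ union s t ↔ y ∈ s ∨ y ∈ t := mem_update s t y
theorem nodup_union (s t : Set α) (h : s.Nodup) : (union s t).Nodup := nodup_update s t h
@[simp] theorem mem_inter (s t : Set α) (y : α) : y ∈ inter s t ↔ y ∈ s ∧ y ∈ t := by simp [inter, contains]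
@[simp] theorem mem_diff (s t : Set α) (y : α) : y ∈ diff s t ↔ y ∈ s ∧ y ∉ t := by simp [diff, contains]
@[simp] theorem mem_discard (s : Set α) (x y : α) : y ∈ discard s x ↔ y ∈ s ∧ y ≠ x := by simp [discard]
omit [LawfulBEq α] in theorem nodup_inter (s t : Set α) (h : s.Nodup) : (inter s t).Nodup := h.filter _
omit [LawfulBEq α] in theorem nodup_diff (s t : Set α) (h : s.Nodup) : (diff s t).Nodup := h.filter _
omit [LawfulBEq α] in theorem nodup_discard (s : Set α) (x : α) (h : s.Nodup) : (discard s x).Nodup := h.filter _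
theorem remove?_eq_none_iff (s : Set α) (x : α) : remove? s x = none ↔ x ∉ s := by simp [remove?, contains]
theorem remove?_of_mem {s : Set α} {x : α} (h : x ∈ s) : remove? s x = some (discard s x) := by simp [remove?, contains, h]
@[simp] theorem issubset_iff (s t : Set α) : issubset s t = true ↔ ∀ x ∈ s, x ∈ t := by simp [issubset, contains]
@[simp] theorem issuperset_iff (s t : Set α) : issuperset s t = true ↔ ∀ x ∈ t, x ∈ s := by simp [issuperset]
/-- Python's s == t: the same members (for proofs: two Nodup lists with the same members are List.Perm — Mathlib's List.perm_ext_iff_of_nodup). -/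
@[simp] theorem equal_iff (s t : Set α) : equal s t = true ↔ ∀ x, x ∈ s ↔ x ∈ t := by
  simp only [equal, Bool.and_eq_true, issubset_iff]
  exact ⟨fun ⟨h1, h2⟩ x => ⟨h1 x, h2 x⟩, fun h => ⟨fun x hx => (h x).mp hx, fun x hx => (h x).mpr hx⟩⟩
@[simp] theorem mem_symmDiff (s t : Set α) (y : α) : y ∈ symmDiff s t ↔ (y ∈ s ∧ y ∉ t) ∨ (y ∈ t ∧ y ∉ s) := by simp [symmDiff]
theorem nodup_symmDiff (s t : Set α) (hs : s.Nodup) (ht : t.Nodup) : (symmDiff s t).Nodup := by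
  rw [symmDiff, _root_.List.nodup_append]
  refine ⟨nodup_diff s t hs, nodup_diff t s ht, ?_⟩
  intro a ha b hb hab; subst hab; rw [mem_diff] at ha hb; exact ha.2 hb.1
@[simp] theorem isdisjoint_iff (s t : Set α) : isdisjoint s t = true ↔ ∀ x ∈ s, x ∉ t := by simp [isdisjoint, contains]
/-- adding fresh, distinct elements appends them. -/
theorem update_eq_append_of_disjoint (s : Set α) (xs : _root_.List α) (hn : xs.Nodup) (hd : ∀ x ∈ xs, x ∉ s) : update s xs = s ++ xs := by
  induction xs generalizing s with
  | nil => simp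
  | cons x t ih =>
    rw [_root_.List.nodup_cons] at hn
    rw [update_cons, add_of_not_mem (hd x _root_.List.mem_cons_self), ih _ hn.2]
    · simp
    · intro y hy hm; rcases _root_.List.mem_append.mp hm with h | h
      · exact hd y (_root_.List.mem_cons_of_mem _ hy) h
      · simp at h; exact hn.1 (h ▸ hy)
theorem ofList_cons_eq_update (y : α) (ys : _root_.List α) : ofList (y :: ys) = update [y] ys := by
  simp [ofList, update_eq_foldl, add]
/-- s.update(xs) is s followed by the NEW elements of xs (first occurrences, in order). -/
theorem update_eq_append_filter (s : Set α) (xs : _root_.List α) : update s xs = s ++ (ofList xs).filter (fun y => !(contains s y)) := by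
  induction xs generalizing s with
  | nil => simp
  | cons y ys ih =>
    rw [update_cons, ih (add s y), ofList_cons_eq_update, ih [y]]
    by_cases hy : y ∈ s
    · rw [add_of_mem hy]
      have h1 : (contains s y) = true := (contains_iff s y).mpr hy
      simp only [_root_.List.cons_append, _root_.List.nil_append, _root_.List.filter_cons, h1, Bool.not_true, Bool.false_eq_true,
        ↓reduceIte, _root_.List.filter_filter]
      congr 1
      apply _root_.List.filter_congr; intro z hz
      by_cases hzy : z = y
      · subst hzy; simp [hy]
      · have : (contains [z] y) = false := by simpa [contains] using fun h => hzy h.symm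
        simp [contains, hzy]
    · rw [add_of_not_mem hy]
      have h1 : (contains s y) = false := by simpa [contains] using hy
      simp only [_root_.List.cons_append, _root_.List.nil_append, _root_.List.filter_cons, h1, Bool.not_false, ↓reduceIte,
        _root_.List.filter_filter, _root_.List.append_assoc]
      congr 1; congr 1
      apply _root_.List.filter_congr; intro z hz
      by_cases hzy : z = y
      · subst hzy; simp [contains]
      · simp [contains, hzy]
/-- set(x :: xs) from the LEFT (for 'induction xs'): x first, then set(xs) without x. -/
theorem ofList_cons (x : α) (xs : _root_.List α) : ofList (x :: xs) = x :: discard (ofList xs) x := by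
  rw [ofList_cons_eq_update, update_eq_append_filter]; simp only [_root_.List.singleton_append, discard]
  congr 1; apply _root_.List.filter_congr; intro z _; simp [contains]
/-- a duplicate-free list is its own set (e.g. set(range(n))). -/
theorem ofList_eq_self_of_nodup (xs : _root_.List α) (h : xs.Nodup) : ofList xs = xs := by
  rw [ofList, ← update_eq_foldl, update_eq_append_of_disjoint _ xs h (by simp)]; rfl
@[simp] theorem ofList_ofList (xs : _root_.List α) : ofList (ofList xs) = ofList xs := ofList_eq_self_of_nodup _ (nodup_ofList xs)
omit [LawfulBEq α] in theorem length_ofList_le (xs : _root_.List α) : (ofList xs).length ≤ xs.length := by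
  suffices h : ∀ (s : Set α), (update s xs).length ≤ s.length + xs.length by simpa [ofList, ← update_eq_foldl] using h []
  induction xs with
  | nil => simp
  | cons x t ih => intro s; rw [update_cons]; refine Nat.le_trans (ih _) ?_; unfold add; split <;> simp <;> omega
end Lawful

/-! ### Lemma pack 4 — set() then update, membership after an add loop -/
/-- 's = set(); s.update(xs)' is set(xs). -/
theorem update_empty (xs : _root_.List α) : update empty xs = ofList xs := rfl
theorem update_nil_left (xs : _root_.List α) : update ([] : Set α) xs = ofList xs := rfl
/-- membership after a loop of s.add(f(b)). -/
theorem mem_foldl_add [LawfulBEq α] {β : Type} (l : _root_.List β) (f : β → α) (s : Set α) (y : α) :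
    y ∈ l.foldl (fun s b => add s (f b)) s ↔ y ∈ s ∨ ∃ b ∈ l, y = f b := by
  induction l generalizing s with
  | nil => simp
  | cons b t ih =>
    simp only [_root_.List.foldl_cons, ih, mem_add, _root_.List.mem_cons]
    constructor
    · rintro ((h | rfl) | ⟨c, hc, rfl⟩)
      · exact Or.inl h
      · exact Or.inr ⟨b, Or.inl rfl, rfl⟩
      · exact Or.inr ⟨c, Or.inr hc, rfl⟩
    · rintro (h | ⟨c, (rfl | hc), rfl⟩)
      · exact Or.inl (Or.inl h)
      · exact Or.inl (Or.inr rfl)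
      · exact Or.inr ⟨c, hc, rfl⟩
/-- s.update(map f l) IS the loop 'for b in l: s.add(f(b))' ('rw [← PySem.Set.update_map_eq_foldl_add]' turns the loop into an update, where mem_update / nodup_update / update_eq_append_… apply). -/
theorem update_map_eq_foldl_add {β : Type} (l : _root_.List β) (f : β → α) (s : Set α) : update s (l.map f) = l.foldl (fun s b => add s (f b)) s := by
  simp [update, _root_.List.foldl_map]
end Set

namespace List
/-- Python 'list(dict.fromkeys(xs))' / the element order of 'set(xs)' here: FIRST occurrences kept, in order (= PySem.Set.ofList).
Always write 'PySem.List.dedup xs' / 'PySem.Set.ofList xs': dot-notation 'xs.dedup' is Mathlib's List.dedup, a DIFFERENT function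
(it keeps LAST occurrences: [1,2,1].dedup = [2,1], whereas dict.fromkeys gives [1,2]). -/
def dedup {α : Type} [BEq α] (xs : _root_.List α) : _root_.List α := Set.ofList xs
@[simp] theorem dedup_eq_ofList {α : Type} [BEq α] (xs : _root_.List α) : dedup xs = Set.ofList xs := rfl
theorem mem_dedup {α : Type} [BEq α] [LawfulBEq α] (xs : _root_.List α) (x : α) : x ∈ dedup xs ↔ x ∈ xs := Set.mem_ofList xs x
theorem nodup_dedup {α : Type} [BEq α] [LawfulBEq α] (xs : _root_.List α) : (dedup xs).Nodup := Set.nodup_ofList xs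
end List

/-! ## Dict — insertion-ordered association list with unique keys -/

/-- Python `dict`: keys unique, iteration in insertion order, overwrite keeps the key's position. -/
structure Dict (κ : Type) (ν : Type) where
  items : _root_.List (κ × ν)
deriving Repr, DecidableEq, BEq

namespace Dict

variable {κ ν : Type} [BEq κ]

def empty : Dict κ ν := ⟨[]⟩
instance : EmptyCollection (Dict κ ν) := ⟨empty⟩
/-- `d.get(k)` / `k in d` lookup; `none` = KeyError for `d[k]`. -/
def get? (d : Dict κ ν) (k : κ) : Option ν := (d.items.find? (fun p => p.1 == k)).map (·.2)
/-- `d.get(k, dflt)`. -/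
def getD (d : Dict κ ν) (k : κ) (dflt : ν) : ν := (d.get? k).getD dflt
def contains (d : Dict κ ν) (k : κ) : Bool := d.items.any (fun p => p.1 == k)
/-- `d[k] = v`: replace in place if present (position kept), else append. -/
def insert (d : Dict κ ν) (k : κ) (v : ν) : Dict κ ν :=
  if d.contains k then ⟨d.items.map fun p => if p.1 == k then (k, v) else p⟩ else ⟨d.items ++ [(k, v)]⟩
/-- `del d[k]` / `d.pop(k)` without the value; absent key leaves d unchanged (use `contains` for KeyError). -/
def erase (d : Dict κ ν) (k : κ) : Dict κ ν := ⟨d.items.filter fun p => !(p.1 == k)⟩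
def pop? (d : Dict κ ν) (k : κ) : Option (ν × Dict κ ν) := (d.get? k).map fun v => (v, d.erase k)
def keys (d : Dict κ ν) : _root_.List κ := d.items.map (·.1)
def values (d : Dict κ ν) : _root_.List ν := d.items.map (·.2)
def size (d : Dict κ ν) : Nat := d.items.length
/-- `d.setdefault(k, v)`. -/
def setdefault (d : Dict κ ν) (k : κ) (v : ν) : Dict κ ν := if d.contains k then d else ⟨d.items ++ [(k, v)]⟩
/-- `d[k] = f(d.get(k, dflt))` — the Counter/accumulate pattern (`d[k] = d.get(k, 0) + 1`). -/
def modify (d : Dict κ ν) (k : κ) (dflt : ν) (f : ν → ν) : Dict κ ν := d.insert k (f (d.getD k dflt))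
/-- `dict(pairs)` / `d.update(pairs)`: later pairs overwrite earlier ones in place. -/
def update (d : Dict κ ν) (ps : _root_.List (κ × ν)) : Dict κ ν := ps.foldl (fun acc p => acc.insert p.1 p.2) d
def ofList (ps : _root_.List (κ × ν)) : Dict κ ν := (empty : Dict κ ν).update ps

@[simp] theorem get?_empty (k : κ) : (empty : Dict κ ν).get? k = none := by simp [get?, empty]
@[simp] theorem getD_empty (k : κ) (d0 : ν) : (empty : Dict κ ν).getD k d0 = d0 := by simp [getD]
@[simp] theorem contains_empty (k : κ) : (empty : Dict κ ν).contains k = false := by simp [contains, empty]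
omit [BEq κ] in @[simp] theorem size_empty : (empty : Dict κ ν).size = 0 := rfl
omit [BEq κ] in @[simp] theorem keys_empty : (empty : Dict κ ν).keys = [] := rfl

-- ---- the bridge lemmas ports kept re-deriving (insert/get?/contains under a lawful BEq)
section Lawful
variable [LawfulBEq κ]

private theorem find?_map_upd_self (l : _root_.List (κ × ν)) (k : κ) (v : ν) (h : l.any (fun p => p.1 == k) = true) :
    (l.map (fun p => if p.1 == k then (k, v) else p)).find? (fun p => p.1 == k) = some (k, v) := by
  induction l with
  | nil => simp at h
  | cons p t ih =>
    simp only [_root_.List.map_cons, _root_.List.find?_cons]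
    by_cases hp : (p.1 == k) = true
    · simp [hp]
    · have hp' : (p.1 == k) = false := by simpa using hp
      have h2 : t.any (fun p => p.1 == k) = true := by
        rw [_root_.List.any_cons, hp'] at h; simpa using h
      simpa [hp'] using ih h2
private theorem find?_map_upd_ne (l : _root_.List (κ × ν)) (k k' : κ) (v : ν) (hne : (k' == k) = false) :
    (l.map (fun p => if p.1 == k then (k, v) else p)).find? (fun p => p.1 == k') = l.find? (fun p => p.1 == k') := by
  induction l with
  | nil => rfl
  | cons p t ih =>
    simp only [_root_.List.map_cons, _root_.List.find?_cons]
    by_cases hp : (p.1 == k) = true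
    · have hpk : p.1 = k := by simpa using hp
      have h1 : (k == k') = false := by
        cases h : (k == k') <;> simp_all [beq_iff_eq]
      have h2 : (p.1 == k') = false := by rw [hpk]; exact h1
      simp [hp, h1, h2, ih]
    · have hp' : (p.1 == k) = false := by simpa using hp
      simp [hp', ih]

/-- `d[k] = v; d[k]` is v. -/
@[simp] theorem get?_insert_self (d : Dict κ ν) (k : κ) (v : ν) : (d.insert k v).get? k = some v := by
  unfold insert get?
  by_cases h : d.contains k = true
  · simp only [h, if_true]; rw [find?_map_upd_self d.items k v (by simpa [contains] using h)]; rfl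
  · have h' : d.contains k = false := by simpa using h
    have hn : d.items.find? (fun p => p.1 == k) = none := by
      rw [_root_.List.find?_eq_none]; intro p hp hpk
      have : d.items.any (fun p => p.1 == k) = true := _root_.List.any_eq_true.mpr ⟨p, hp, hpk⟩
      simp [contains, this] at h'
    simp [h', _root_.List.find?_append, hn]
/-- `d[k] = v` leaves every other key's value alone. -/
theorem get?_insert_of_ne (d : Dict κ ν) {k k' : κ} (v : ν) (hne : k' ≠ k) : (d.insert k v).get? k' = d.get? k' := by
  have hb : (k' == k) = false := by simpa [beq_iff_eq] using hne
  unfold insert get?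
  by_cases h : d.contains k = true
  · simp only [h, if_true]; rw [find?_map_upd_ne d.items k k' v hb]
  · have h' : d.contains k = false := by simpa using h
    have hb2 : (k == k') = false := by cases hh : (k == k') <;> simp_all [beq_iff_eq]
    simp [h', _root_.List.find?_append, hb2]
@[simp] theorem getD_insert_self (d : Dict κ ν) (k : κ) (v d0 : ν) : (d.insert k v).getD k d0 = v := by simp [getD]
theorem getD_insert_of_ne (d : Dict κ ν) {k k' : κ} (v d0 : ν) (hne : k' ≠ k) : (d.insert k v).getD k' d0 = d.getD k' d0 := by
  simp [getD, get?_insert_of_ne d v hne]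
@[simp] theorem contains_insert_self (d : Dict κ ν) (k : κ) (v : ν) : (d.insert k v).contains k = true := by
  have := get?_insert_self d k v
  unfold get? at this
  cases hf : (d.insert k v).items.find? (fun p => p.1 == k) with
  | none => simp [hf] at this
  | some p =>
    have := _root_.List.find?_some hf
    exact _root_.List.any_eq_true.mpr ⟨p, _root_.List.mem_of_find?_eq_some hf, this⟩
theorem get?_eq_none_iff_contains (d : Dict κ ν) (k : κ) : d.get? k = none ↔ d.contains k = false := by
  simp only [get?, Option.map_eq_none_iff, _root_.List.find?_eq_none, contains]
  constructor
  · intro h; apply Bool.eq_false_iff.mpr; intro ha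
    obtain ⟨p, hp, hk⟩ := _root_.List.any_eq_true.mp ha; exact absurd hk (by simpa using h p hp)
  · intro h p hp hk
    have : d.items.any (fun p => p.1 == k) = true := _root_.List.any_eq_true.mpr ⟨p, hp, hk⟩
    simp [this] at h
/-- The Counter pattern: `d[k] = d.get(k, 0) + 1` then reading k. -/
@[simp] theorem getD_modify_self (d : Dict κ ν) (k : κ) (d0 : ν) (f : ν → ν) : (d.modify k d0 f).getD k d0 = f (d.getD k d0) := by
  simp [modify]
theorem getD_modify_of_ne (d : Dict κ ν) {k k' : κ} (d0 : ν) (f : ν → ν) (hne : k' ≠ k) : (d.modify k d0 f).getD k' d0 = d.getD k' d0 := by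
  simp [modify, getD_insert_of_ne d _ d0 hne]
omit [LawfulBEq κ] in
private theorem any_key_iff (l : _root_.List (κ × ν)) (k : κ) [LawfulBEq κ] : l.any (fun p => p.1 == k) = true ↔ k ∈ l.map (·.1) := by
  induction l with
  | nil => simp
  | cons p t ih =>
    simp only [_root_.List.any_cons, Bool.or_eq_true, _root_.List.map_cons, _root_.List.mem_cons, ih, beq_iff_eq]
    constructor <;> rintro (h | h) <;> simp_all
/-- `k in d` ↔ k is one of the keys. -/
theorem contains_iff_mem_keys (d : Dict κ ν) (k : κ) : d.contains k = true ↔ k ∈ d.keys := any_key_iff d.items k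
/-- after `d[k] = v`, a key k' is present iff it is k or was present. -/
theorem contains_insert (d : Dict κ ν) (k k' : κ) (v : ν) : (d.insert k v).contains k' = (k' == k || d.contains k') := by
  by_cases hk : k' = k
  · subst hk; simp
  · have hb : (k' == k) = false := by simpa [beq_iff_eq] using hk
    rw [hb, Bool.false_or]
    have h1 := get?_insert_of_ne d v hk
    cases hc : d.contains k' with
    | false =>
      have : d.get? k' = none := (get?_eq_none_iff_contains d k').mpr hc
      exact (get?_eq_none_iff_contains _ k').mp (h1.trans this)
    | true =>
      cases hf : (d.insert k v).contains k' with
      | true => rfl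
      | false =>
        exfalso
        have := (get?_eq_none_iff_contains _ k').mpr hf
        rw [h1] at this
        have := (get?_eq_none_iff_contains d k').mp this
        simp [hc] at this
theorem mem_keys_insert (d : Dict κ ν) (k k' : κ) (v : ν) : k' ∈ (d.insert k v).keys ↔ k' = k ∨ k' ∈ d.keys := by
  rw [← contains_iff_mem_keys, contains_insert, Bool.or_eq_true, ← contains_iff_mem_keys]; simp [beq_iff_eq]
omit [LawfulBEq κ] in @[simp] theorem keys_modify (d : Dict κ ν) (k : κ) (d0 : ν) (f : ν → ν) : (d.modify k d0 f).keys = (d.insert k (f (d.getD k d0))).keys := rfl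
theorem contains_modify (d : Dict κ ν) (k k' : κ) (d0 : ν) (f : ν → ν) : (d.modify k d0 f).contains k' = (k' == k || d.contains k') := by
  simp [modify, contains_insert]
omit [LawfulBEq κ] in
private theorem find?_key_of_mem (l : _root_.List (κ × ν)) {k : κ} {v : ν} [LawfulBEq κ] (h : (k, v) ∈ l) (hnd : (l.map (·.1)).Nodup) :
    (l.find? (fun p => p.1 == k)).map (·.2) = some v := by
  induction l with
  | nil => simp at h
  | cons p t ih =>
    simp only [_root_.List.map_cons, _root_.List.nodup_cons] at hnd
    rcases _root_.List.mem_cons.mp h with hp | ht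
    · subst hp; simp
    · have hne : ¬ (p.1 == k) = true := by
        intro hb; have : p.1 = k := by simpa using hb
        exact hnd.1 (this ▸ _root_.List.mem_map.mpr ⟨(k, v), ht, rfl⟩)
      have hf : (p.1 == k) = false := by simpa using hne
      simp only [_root_.List.find?_cons, hf]
      exact ih ht hnd.2
/-- a pair in the items list is what get? returns for its key, provided keys are unique (true for every Dict built by insert/ofList/update
from empty: see nodup_keys_*). -/
theorem get?_of_mem_items (d : Dict κ ν) {k : κ} {v : ν} (h : (k, v) ∈ d.items) (hnd : d.keys.Nodup) : d.get? k = some v :=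
  find?_key_of_mem d.items h (by simpa [keys] using hnd)
end Lawful

theorem size_insert (d : Dict κ ν) (k : κ) (v : ν) : (d.insert k v).size = if d.contains k then d.size else d.size + 1 := by
  unfold insert size; split <;> simp

theorem keys_insert_of_not_contains (d : Dict κ ν) {k : κ} (v : ν) (h : d.contains k = false) :
    (d.insert k v).keys = d.keys ++ [k] := by
  simp [insert, h, keys]
theorem keys_insert_of_contains (d : Dict κ ν) {k : κ} (v : ν) (h : d.contains k = true) [LawfulBEq κ] :
    (d.insert k v).keys = d.keys := by
  simp only [insert, h, if_true, keys, _root_.List.map_map]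
  apply _root_.List.map_congr_left; intro p _
  by_cases hp : (p.1 == k) = true
  · have : p.1 = k := by simpa using hp
    simp [this]
  · have hp' : (p.1 == k) = false := by simpa using hp
    simp [hp']

theorem nodup_keys_insert [LawfulBEq κ] (d : Dict κ ν) (k : κ) (v : ν) (h : d.keys.Nodup) : (d.insert k v).keys.Nodup := by
  by_cases hc : d.contains k = true
  · rw [keys_insert_of_contains d v hc]; exact h
  · have hc' : d.contains k = false := by simpa using hc
    rw [keys_insert_of_not_contains d v hc', _root_.List.nodup_append]
    refine ⟨h, by simp, ?_⟩
    intro a ha b hb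
    simp at hb; subst hb
    intro hak; subst hak
    exact absurd ((contains_iff_mem_keys d a).mpr ha) (by simp [hc'])
theorem nodup_keys_update [LawfulBEq κ] (d : Dict κ ν) (ps : _root_.List (κ × ν)) (h : d.keys.Nodup) : (d.update ps).keys.Nodup := by
  unfold update
  induction ps generalizing d with
  | nil => simpa
  | cons p t ih => simp only [_root_.List.foldl_cons]; exact ih _ (nodup_keys_insert d p.1 p.2 h)
@[simp] theorem nodup_keys_ofList [LawfulBEq κ] (ps : _root_.List (κ × ν)) : (ofList ps : Dict κ ν).keys.Nodup := nodup_keys_update _ ps (by simp [keys, empty])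
omit [BEq κ] in @[simp] theorem nodup_keys_empty : (empty : Dict κ ν).keys.Nodup := by simp


-- ---- lemma pack 3: getD / get? after insert in 'if' form, items after insert, the Counter pattern, keys of a fold of inserts
theorem getD_eq_get?_getD (d : Dict κ ν) (k : κ) (d0 : ν) : d.getD k d0 = (d.get? k).getD d0 := rfl
theorem getD_of_get?_eq_some (d : Dict κ ν) {k : κ} {v : ν} (d0 : ν) (h : d.get? k = some v) : d.getD k d0 = v := by simp [getD, h]
theorem getD_of_get?_eq_none (d : Dict κ ν) {k : κ} (d0 : ν) (h : d.get? k = none) : d.getD k d0 = d0 := by simp [getD, h]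
/-- the items list after d[k] = v, both cases at once. -/
theorem items_insert (d : Dict κ ν) (k : κ) (v : ν) :
    (d.insert k v).items = if d.contains k then d.items.map (fun p => if p.1 == k then (k, v) else p) else d.items ++ [(k, v)] := by
  unfold insert; split <;> rfl
theorem items_insert_of_not_contains (d : Dict κ ν) {k : κ} (v : ν) (h : d.contains k = false) : (d.insert k v).items = d.items ++ [(k, v)] := by
  simp [items_insert, h]
theorem items_insert_of_contains (d : Dict κ ν) {k : κ} (v : ν) (h : d.contains k = true) :
    (d.insert k v).items = d.items.map (fun p => if p.1 == k then (k, v) else p) := by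
  simp [items_insert, h]
/-- a literal dict read at its head pair. -/
theorem get?_mk_cons (k : κ) (v : ν) (rest : _root_.List (κ × ν)) (x : κ) :
    (Dict.mk ((k, v) :: rest)).get? x = if k == x then some v else (Dict.mk rest).get? x := by
  simp only [get?, _root_.List.find?_cons]; split <;> simp_all
@[simp] theorem contains_mk (ps : _root_.List (κ × ν)) (k : κ) : (Dict.mk ps).contains k = ps.any (fun p => p.1 == k) := rfl
omit [BEq κ] in @[simp] theorem keys_mk (ps : _root_.List (κ × ν)) : (Dict.mk ps).keys = ps.map (·.1) := rfl
omit [BEq κ] in @[simp] theorem values_mk (ps : _root_.List (κ × ν)) : (Dict.mk ps).values = ps.map (·.2) := rfl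
/-- 'k in d' through the lookup. (rw-only — kept out of the `pysem` simp set, where with get?_eq_none_iff_contains and core's Option.isSome_eq_false_iff
it would cycle; inside the set `contains` normalises to keys-membership instead.) -/
theorem contains_eq_isSome_get? (d : Dict κ ν) (k : κ) : d.contains k = (d.get? k).isSome := by
  obtain ⟨items⟩ := d
  simp only [contains, get?, Option.isSome_map]
  induction items with
  | nil => rfl
  | cons p t ih => simp only [_root_.List.any_cons, _root_.List.find?_cons]; cases hp : (p.1 == k) <;> simp [ih]
theorem getD_of_not_contains (d : Dict κ ν) {k : κ} (d0 : ν) (h : d.contains k = false) : d.getD k d0 = d0 := by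
  rw [contains_eq_isSome_get?] at h; cases hg : d.get? k <;> simp_all [getD]

section Lawful3
variable [LawfulBEq κ]
/-- d[k] = v then d.get(k'), as one 'if'. -/
theorem get?_insert [DecidableEq κ] (d : Dict κ ν) (k k' : κ) (v : ν) : (d.insert k v).get? k' = if k' = k then some v else d.get? k' := by
  split
  · subst_vars; exact get?_insert_self d _ v
  · exact get?_insert_of_ne d v (by assumption)
theorem getD_insert [DecidableEq κ] (d : Dict κ ν) (k k' : κ) (v d0 : ν) : (d.insert k v).getD k' d0 = if k' = k then v else d.getD k' d0 := by
  split
  · subst_vars; exact getD_insert_self d _ v d0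
  · exact getD_insert_of_ne d v d0 (by assumption)
theorem getD_modify [DecidableEq κ] (d : Dict κ ν) (k k' : κ) (d0 : ν) (f : ν → ν) :
    (d.modify k d0 f).getD k' d0 = if k' = k then f (d.getD k d0) else d.getD k' d0 := by
  split
  · subst_vars; exact getD_modify_self d _ d0 f
  · exact getD_modify_of_ne d d0 f (by assumption)
theorem contains_eq_decide_mem_keys [DecidableEq κ] (d : Dict κ ν) (k : κ) : d.contains k = decide (k ∈ d.keys) := by
  apply Bool.eq_iff_iff.mpr; rw [contains_iff_mem_keys]; simp
/-- membership in the items after d[k] = v: the new pair, or an old pair with another key. -/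
theorem mem_items_insert (d : Dict κ ν) (k : κ) (v : ν) (p : κ × ν) :
    p ∈ (d.insert k v).items ↔ p = (k, v) ∨ (p ∈ d.items ∧ p.1 ≠ k) := by
  rw [items_insert]; split
  · rename_i hc
    rw [_root_.List.mem_map]
    constructor
    · rintro ⟨q, hq, rfl⟩
      cases hqk : (q.1 == k)
      · right; simp only [Bool.false_eq_true, ↓reduceIte]; exact ⟨hq, by simpa using hqk⟩
      · left; simp
    · rintro (rfl | ⟨hp, hne⟩)
      · have hc' : d.items.any (fun p => p.1 == k) = true := hc
        obtain ⟨q, hq, hqk⟩ := _root_.List.any_eq_true.mp hc'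
        exact ⟨q, hq, by simp [hqk]⟩
      · have hb : (p.1 == k) = false := by simpa using hne
        exact ⟨p, hp, by simp [hb]⟩
  · rename_i hc
    have hc' : d.contains k = false := by simpa using hc
    rw [_root_.List.mem_append, _root_.List.mem_singleton]
    constructor
    · rintro (hp | rfl)
      · right; refine ⟨hp, fun hpk => ?_⟩
        have : d.contains k = true := _root_.List.any_eq_true.mpr ⟨p, hp, by simp [hpk]⟩
        simp [hc'] at this
      · exact Or.inl rfl
    · rintro (rfl | ⟨hp, _⟩)
      · exact Or.inr rfl
      · exact Or.inl hp
theorem mem_items_insert_self (d : Dict κ ν) (k : κ) (v : ν) : (k, v) ∈ (d.insert k v).items := (mem_items_insert d k v _).mpr (Or.inl rfl)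
/-- a value after d[k] = v is v or an old value. -/
theorem mem_values_insert (d : Dict κ ν) (k : κ) (v w : ν) (h : w ∈ (d.insert k v).values) : w = v ∨ w ∈ d.values := by
  simp only [values, _root_.List.mem_map] at h ⊢
  obtain ⟨p, hp, rfl⟩ := h
  rcases (mem_items_insert d k v p).mp hp with rfl | ⟨hp', _⟩
  · exact Or.inl rfl
  · exact Or.inr ⟨p, hp', rfl⟩
/-- what get? returns is an item (no uniqueness needed in this direction). -/
theorem mem_items_of_get?_eq_some (d : Dict κ ν) {k : κ} {v : ν} (h : d.get? k = some v) : (k, v) ∈ d.items := by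
  simp only [get?, Option.map_eq_some_iff] at h
  obtain ⟨p, hp, rfl⟩ := h
  have hk : p.1 = k := by simpa using _root_.List.find?_some hp
  exact hk ▸ _root_.List.mem_of_find?_eq_some hp
theorem get?_eq_some_iff_mem_items (d : Dict κ ν) (k : κ) (v : ν) (hnd : d.keys.Nodup) : d.get? k = some v ↔ (k, v) ∈ d.items :=
  ⟨mem_items_of_get?_eq_some d, fun h => get?_of_mem_items d h hnd⟩
theorem getD_of_mem_items (d : Dict κ ν) {k : κ} {v : ν} (h : (k, v) ∈ d.items) (hnd : d.keys.Nodup) (d0 : ν) : d.getD k d0 = v := by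
  simp [getD, get?_of_mem_items d h hnd]
omit [BEq κ] [LawfulBEq κ] in theorem mem_keys_of_mem_items (d : Dict κ ν) {p : κ × ν} (h : p ∈ d.items) : p.1 ∈ d.keys := _root_.List.mem_map.mpr ⟨p, h, rfl⟩
theorem get?_eq_none_iff_not_mem_keys (d : Dict κ ν) (k : κ) : d.get? k = none ↔ k ∉ d.keys := by
  rw [get?_eq_none_iff_contains, ← contains_iff_mem_keys]; simp
/-- the keys after a loop of 'd[x] = …' over l are d's keys updated, AS A SET, with l (whatever the values). -/
theorem keys_foldl_insert (l : _root_.List κ) (f : Dict κ ν → κ → ν) (d : Dict κ ν) :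
    (l.foldl (fun d x => d.insert x (f d x)) d).keys = Set.update d.keys l := by
  induction l generalizing d with
  | nil => rfl
  | cons x t ih =>
    simp only [_root_.List.foldl_cons, Set.update_cons, ih]
    congr 1
    cases hc : d.contains x with
    | true => rw [keys_insert_of_contains d _ hc, Set.add_of_mem ((contains_iff_mem_keys d x).mp hc)]
    | false =>
      rw [keys_insert_of_not_contains d _ hc, Set.add_of_not_mem]
      rw [← contains_iff_mem_keys]; simp [hc]
/-- the same for a loop inserting under a key COMPUTED from the element ('for p in l: d[p[0]] = …'). -/
theorem keys_foldl_insert_key {β : Type} (l : _root_.List β) (key : β → κ) (f : Dict κ ν → β → ν) (d : Dict κ ν) :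
    (l.foldl (fun d x => d.insert (key x) (f d x)) d).keys = Set.update d.keys (l.map key) := by
  induction l generalizing d with
  | nil => rfl
  | cons x t ih =>
    simp only [_root_.List.foldl_cons, _root_.List.map_cons, Set.update_cons, ih]
    congr 1
    cases hc : d.contains (key x) with
    | true => rw [keys_insert_of_contains d _ hc, Set.add_of_mem ((contains_iff_mem_keys d _).mp hc)]
    | false =>
      rw [keys_insert_of_not_contains d _ hc, Set.add_of_not_mem]
      rw [← contains_iff_mem_keys]; simp [hc]
theorem keys_foldl_modify_key {β : Type} (l : _root_.List β) (key : β → κ) (d0 : ν) (f : Dict κ ν → β → ν → ν) (d : Dict κ ν) :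
    (l.foldl (fun d x => d.modify (key x) d0 (f d x)) d).keys = Set.update d.keys (l.map key) := keys_foldl_insert_key l key _ d
theorem keys_foldl_modify (l : _root_.List κ) (d0 : ν) (f : Dict κ ν → κ → ν → ν) (d : Dict κ ν) :
    (l.foldl (fun d x => d.modify x d0 (f d x)) d).keys = Set.update d.keys l := keys_foldl_insert l _ d
/-- THE COUNTER LOOP: 'for x in l: d[x] = d.get(x, 0) + 1' then 'd.get(v, 0)' is the old value plus l.count(v)  (Int / Nat values). -/
theorem getD_foldl_modify_add_one (l : _root_.List κ) (d : Dict κ _root_.Int) (v : κ) :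
    (l.foldl (fun d x => d.modify x 0 (· + 1)) d).getD v 0 = d.getD v 0 + (l.count v : _root_.Int) := by
  induction l generalizing d with
  | nil => simp
  | cons x t ih =>
    simp only [_root_.List.foldl_cons, ih, _root_.List.count_cons]
    by_cases h : v = x
    · subst h; rw [getD_modify_self]; simp; omega
    · rw [getD_modify_of_ne d 0 _ h]; have : (x == v) = false := by simpa [beq_iff_eq] using Ne.symm h
      simp [this]
theorem getD_foldl_insert_add_one (l : _root_.List κ) (d : Dict κ _root_.Int) (v : κ) :
    (l.foldl (fun d x => d.insert x (d.getD x 0 + 1)) d).getD v 0 = d.getD v 0 + (l.count v : _root_.Int) :=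
  getD_foldl_modify_add_one l d v
theorem getD_foldl_modify_add_one_nat (l : _root_.List κ) (d : Dict κ Nat) (v : κ) :
    (l.foldl (fun d x => d.modify x 0 (· + 1)) d).getD v 0 = d.getD v 0 + l.count v := by
  induction l generalizing d with
  | nil => simp
  | cons x t ih =>
    simp only [_root_.List.foldl_cons, ih, _root_.List.count_cons]
    by_cases h : v = x
    · subst h; rw [getD_modify_self]; simp; omega
    · rw [getD_modify_of_ne d 0 _ h]; have : (x == v) = false := by simpa [beq_iff_eq] using Ne.symm h
      simp [this]
/-- the grouping loop: 'for (k, x) in l: d[k] = d.get(k, []) + [x]' then 'd.get(c, [])'. -/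
theorem getD_foldl_modify_append {β : Type} (l : _root_.List (κ × β)) (d : Dict κ (_root_.List β)) (c : κ) :
    (l.foldl (fun d p => d.modify p.1 [] (· ++ [p.2])) d).getD c [] = d.getD c [] ++ (l.filter (fun p => p.1 == c)).map (·.2) := by
  induction l generalizing d with
  | nil => simp
  | cons p t ih =>
    simp only [_root_.List.foldl_cons, ih, _root_.List.filter_cons]
    by_cases h : c = p.1
    · subst h; rw [getD_modify_self]; simp
    · rw [getD_modify_of_ne d [] _ h]; have : (p.1 == c) = false := by simpa [beq_iff_eq] using Ne.symm h
      simp [this]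
end Lawful3

/-- Python 'collections.Counter(xs)' / the counting-dict idiom, as a Dict κ Int in first-occurrence key order. -/
def counter (xs : _root_.List κ) : Dict κ _root_.Int := xs.foldl (fun d x => d.modify x 0 (· + 1)) empty
theorem counter_eq_foldl (xs : _root_.List κ) : counter xs = xs.foldl (fun d x => d.modify x 0 (· + 1)) empty := rfl
/-- the insert-spelled counting loop IS counter (definitionally), so it rewrites to counter in one step. -/
theorem foldl_insert_getD_add_one_eq_counter (xs : _root_.List κ) : xs.foldl (fun d x => d.insert x (d.getD x 0 + 1)) empty = counter xs := rfl
theorem counter_append_singleton (xs : _root_.List κ) (x : κ) : counter (xs ++ [x]) = (counter xs).modify x 0 (· + 1) := by simp [counter]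
@[simp] theorem getD_counter [LawfulBEq κ] (xs : _root_.List κ) (v : κ) : (counter xs).getD v 0 = (xs.count v : _root_.Int) := by
  rw [counter, getD_foldl_modify_add_one]; simp
@[simp] theorem keys_counter [LawfulBEq κ] (xs : _root_.List κ) : (counter xs).keys = Set.ofList xs := by
  rw [counter, keys_foldl_modify]; rfl
theorem contains_counter [LawfulBEq κ] (xs : _root_.List κ) (v : κ) : (counter xs).contains v = xs.contains v := by
  apply Bool.eq_iff_iff.mpr; rw [contains_iff_mem_keys, keys_counter, Set.mem_ofList]; simp
theorem nodup_keys_counter [LawfulBEq κ] (xs : _root_.List κ) : (counter xs).keys.Nodup := by rw [keys_counter]; exact Set.nodup_ofList xs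
/-- Counter(xs).items(): each distinct element (first-occurrence order) with its count — the port of a function RETURNING a Counter. -/
theorem items_counter [LawfulBEq κ] (xs : _root_.List κ) : (counter xs).items = (Set.ofList xs).map (fun k => (k, (xs.count k : _root_.Int))) := by
  suffices H : ∀ (ys : _root_.List κ), (counter ys.reverse).items = (Set.ofList ys.reverse).map (fun k => (k, (ys.reverse.count k : _root_.Int))) by
    simpa using H xs.reverse
  intro ys
  induction ys with
  | nil => rfl
  | cons x u ih =>
    rw [_root_.List.reverse_cons]
    generalize u.reverse = t at ih ⊢
    rw [counter_append_singleton, Set.ofList_append_singleton, modify, items_insert]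
    have hg : (counter t).getD x 0 = (t.count x : _root_.Int) := getD_counter t x
    cases hc : (counter t).contains x with
    | true =>
      have hx : x ∈ Set.ofList t := by rw [← keys_counter]; exact (contains_iff_mem_keys _ _).mp hc
      simp only [↓reduceIte, ih, _root_.List.map_map, Set.add_of_mem hx, hg]
      apply _root_.List.map_congr_left; intro k hk
      by_cases hkx : k = x
      · subst hkx; simp [_root_.List.count_append]
      · have hb : (k == x) = false := by simpa using hkx
        have hb' : (x == k) = false := by simpa using (Ne.symm hkx)
        simp [hb, hb', _root_.List.count_append, _root_.List.count_cons]
    | false =>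
      have hx : x ∉ Set.ofList t := by rw [← keys_counter, ← contains_iff_mem_keys]; simp [hc]
      have hx' : x ∉ t := fun h => hx ((Set.mem_ofList t x).mpr h)
      simp only [Bool.false_eq_true, ↓reduceIte, ih, Set.add_of_not_mem hx, _root_.List.map_append, _root_.List.map_cons, _root_.List.map_nil, hg]
      congr 1
      · apply _root_.List.map_congr_left; intro k hk
        have hkx : k ≠ x := fun e => hx (e ▸ hk)
        have hb' : (x == k) = false := by simpa using (Ne.symm hkx)
        simp [_root_.List.count_append, _root_.List.count_cons, hb']
      · simp [_root_.List.count_append]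


/-! ### Lemma pack 4 — dict extensionality and items/keys/values, d[k]=v twice / in either order, setdefault, fresh-key insert loops, Nodup keys through loops -/
section Pack4
/- two dicts with the same items are equal: `attribute [ext]` generates `Dict.ext (h : d.items = d'.items) : d = d'` and `Dict.ext_iff`
   (generated, not stated, so the variable-headed `ext` stays out of the `pysem` simp set). -/
attribute [ext] Dict
private theorem setdefault_eq_ite (d : Dict κ ν) (k : κ) (v : ν) : d.setdefault k v = if d.contains k then d else d.insert k v := by
  unfold setdefault insert; split <;> simp_all
/-- d.setdefault(k, v) is 'if k in d: pass else: d[k] = v' — a present key leaves d alone, an absent one is d[k] = v (then every insert lemma applies). -/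
theorem setdefault_of_contains (d : Dict κ ν) {k : κ} (v : ν) (h : d.contains k = true) : d.setdefault k v = d := by
  simp [setdefault_eq_ite, h]
theorem setdefault_of_not_contains (d : Dict κ ν) {k : κ} (v : ν) (h : d.contains k = false) : d.setdefault k v = d.insert k v := by
  simp [setdefault_eq_ite, h]
variable [LawfulBEq κ]
/-- d[k] = v; d[k] = w is d[k] = w. -/
theorem insert_insert_self (d : Dict κ ν) (k : κ) (v w : ν) : (d.insert k v).insert k w = d.insert k w := by
  apply Dict.ext
  rw [items_insert_of_contains _ _ (contains_insert_self d k v), items_insert, items_insert]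
  split
  · rw [_root_.List.map_map]; apply _root_.List.map_congr_left; intro p _
    by_cases hp : (p.1 == k) = true <;> simp [hp]
  · rename_i hc
    rw [_root_.List.map_append, _root_.List.map_cons, _root_.List.map_nil]
    simp only [BEq.rfl, ↓reduceIte]
    congr 1
    conv => rhs; rw [← _root_.List.map_id d.items]
    apply _root_.List.map_congr_left; intro p hp
    have : (p.1 == k) = false := by
      apply Bool.eq_false_iff.mpr; intro hpk
      exact hc (_root_.List.any_eq_true.mpr ⟨p, hp, hpk⟩)
    simp [this]
/-- d[k] = v; d[k'] = v' for k ≠ k' READ the same either way round (the items lists differ in order — insertion order — so only lookups commute). -/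
theorem get?_insert_insert_comm [DecidableEq κ] (d : Dict κ ν) {k k' : κ} (v v' : ν) (hne : k ≠ k') (j : κ) :
    ((d.insert k v).insert k' v').get? j = ((d.insert k' v').insert k v).get? j := by
  simp only [get?_insert]; split <;> split <;> simp_all
theorem getD_insert_insert_comm [DecidableEq κ] (d : Dict κ ν) {k k' : κ} (v v' : ν) (hne : k ≠ k') (j : κ) (d0 : ν) :
    ((d.insert k v).insert k' v').getD j d0 = ((d.insert k' v').insert k v).getD j d0 := by
  simp only [getD, get?_insert_insert_comm d v v' hne]
theorem contains_insert_insert_comm (d : Dict κ ν) (k k' : κ) (v v' : ν) (j : κ) :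
    ((d.insert k v).insert k' v').contains j = ((d.insert k' v').insert k v).contains j := by
  simp only [contains_insert]; cases (j == k) <;> cases (j == k') <;> simp
/-- the keys stay duplicate-free through any loop of d[key(x)] = … (start from a dict with Nodup keys, e.g. empty / ofList / counter). -/
theorem nodup_keys_foldl_insert_key {β : Type} (l : _root_.List β) (key : β → κ) (f : Dict κ ν → β → ν) (d : Dict κ ν) (h : d.keys.Nodup) :
    (l.foldl (fun d x => d.insert (key x) (f d x)) d).keys.Nodup := by
  rw [keys_foldl_insert_key]; exact Set.nodup_update _ _ h
theorem nodup_keys_foldl_insert (l : _root_.List κ) (f : Dict κ ν → κ → ν) (d : Dict κ ν) (h : d.keys.Nodup) :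
    (l.foldl (fun d x => d.insert x (f d x)) d).keys.Nodup := by
  rw [keys_foldl_insert]; exact Set.nodup_update _ _ h
theorem nodup_keys_foldl_modify_key {β : Type} (l : _root_.List β) (key : β → κ) (d0 : ν) (f : Dict κ ν → β → ν → ν) (d : Dict κ ν) (h : d.keys.Nodup) :
    (l.foldl (fun d x => d.modify (key x) d0 (f d x)) d).keys.Nodup := nodup_keys_foldl_insert_key l key _ d h
/-- d.items() / d.values() read through the keys: each key paired with its looked-up value (keys unique). -/
theorem items_eq_map_keys (d : Dict κ ν) (hnd : d.keys.Nodup) (dflt : ν) : d.items = d.keys.map (fun k => (k, d.getD k dflt)) := by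
  rw [keys, _root_.List.map_map]
  conv => lhs; rw [← _root_.List.map_id d.items]
  apply _root_.List.map_congr_left; intro p hp
  obtain ⟨k, v⟩ := p
  simp [getD_of_mem_items d hp hnd dflt]
theorem values_eq_map_keys (d : Dict κ ν) (hnd : d.keys.Nodup) (dflt : ν) : d.values = d.keys.map (fun k => d.getD k dflt) := by
  rw [values, items_eq_map_keys d hnd dflt, _root_.List.map_map]; rfl
/-- a loop d[k(a)] = v(a) over FRESH, pairwise-distinct keys appends its pairs in order. -/
theorem items_foldl_insert_fresh {β : Type} (l : _root_.List β) (k : β → κ) (v : β → ν) (d : Dict κ ν)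
    (hdis : ∀ a ∈ l, d.contains (k a) = false) (hnd : (l.map k).Nodup) :
    (l.foldl (fun d a => d.insert (k a) (v a)) d).items = d.items ++ l.map (fun a => (k a, v a)) := by
  induction l generalizing d with
  | nil => simp
  | cons a t ih =>
    rw [_root_.List.map_cons, _root_.List.nodup_cons] at hnd
    rw [_root_.List.foldl_cons, ih _ _ hnd.2, items_insert_of_not_contains d _ (hdis a _root_.List.mem_cons_self)]
    · simp
    · intro b hb
      rw [contains_insert, hdis b (_root_.List.mem_cons_of_mem _ hb), Bool.or_false]
      have : k b ≠ k a := fun e => hnd.1 (e ▸ _root_.List.mem_map.mpr ⟨b, hb, rfl⟩)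
      simpa using this
theorem get?_setdefault_self (d : Dict κ ν) (k : κ) (v : ν) : (d.setdefault k v).get? k = some ((d.get? k).getD v) := by
  rw [setdefault_eq_ite]; split
  · rename_i h; rw [contains_eq_isSome_get?] at h
    cases hg : d.get? k with
    | none => simp [hg] at h
    | some w => rfl
  · rename_i h
    have h' : d.contains k = false := by simpa using h
    rw [get?_insert_self, (get?_eq_none_iff_contains d k).mpr h']; rfl
theorem get?_setdefault_of_ne (d : Dict κ ν) {k k' : κ} (v : ν) (hne : k' ≠ k) : (d.setdefault k v).get? k' = d.get? k' := by
  rw [setdefault_eq_ite]; split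
  · rfl
  · exact get?_insert_of_ne d v hne
theorem getD_setdefault_self (d : Dict κ ν) (k : κ) (v d0 : ν) : (d.setdefault k v).getD k d0 = d.getD k v := by
  simp [getD, get?_setdefault_self]
theorem contains_setdefault (d : Dict κ ν) (k k' : κ) (v : ν) : (d.setdefault k v).contains k' = (k' == k || d.contains k') := by
  rw [setdefault_eq_ite]; split
  · rename_i h; cases hk : (k' == k)
    · simp
    · have : k' = k := by simpa using hk
      subst this; simp [h]
  · exact contains_insert d k k' v
omit [LawfulBEq κ] in
theorem keys_setdefault (d : Dict κ ν) (k : κ) (v : ν) : (d.setdefault k v).keys = if d.contains k then d.keys else d.keys ++ [k] := by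
  rw [setdefault_eq_ite]; split
  · rfl
  · rename_i h; exact keys_insert_of_not_contains d v (by simpa using h)
end Pack4

end Dict

/-! ## Chars / Str — Python's whitespace/digit/letter sets and split/strip, exact on printable ASCII + the ASCII controls.
Every function is DEFINED on `List Char` in `PySem.Chars` (kernel-transparent); `PySem.Str` has the same names on `String`
as thin wrappers (`f s = … (Chars.f s.toList)`), each with a `@[simp]` bridge lemma, so a proof moves to the list form in one
`simp` and never meets Lean's opaque String internals. -/
namespace Chars

/-- `c.isspace()` — Python's set. Exact for code points below 128 (space \t \n \r \x0b \x0c \x1c \x1d \x1e \x1f) and for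
U+0085/U+00A0/U+1680/U+2000–200A/U+2028/U+2029/U+202F/U+205F/U+3000 (the rest of Unicode White_Space). -/
def isspace (c : Char) : Bool :=
  let n := c.toNat
  n = 32 || (9 ≤ n && n ≤ 13) || (28 ≤ n && n ≤ 31) || n = 0x85 || n = 0xA0 || n = 0x1680 ||
  (0x2000 ≤ n && n ≤ 0x200A) || n = 0x2028 || n = 0x2029 || n = 0x202F || n = 0x205F || n = 0x3000
/-- `c.isdigit()` on ASCII (Unicode digits such as '²' or '٣' are outside the stated domain). -/
def isdigit (c : Char) : Bool := '0' ≤ c && c ≤ '9'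
def isupper (c : Char) : Bool := 'A' ≤ c && c ≤ 'Z'
def islower (c : Char) : Bool := 'a' ≤ c && c ≤ 'z'
/-- `c.isalpha()` on ASCII. -/
def isalpha (c : Char) : Bool := isupper c || islower c
def isalnum (c : Char) : Bool := isalpha c || isdigit c
/-- ASCII case mapping of one character (Python's str.lower/upper restricted to the stated domain). -/
def lowerChar (c : Char) : Char := if isupper c then Char.ofNat (c.toNat + 32) else c
def upperChar (c : Char) : Char := if islower c then Char.ofNat (c.toNat - 32) else c

/-- `s.isdigit()` etc. on a whole string: non-empty and every character qualifies. -/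
def strIsdigit (s : _root_.List Char) : Bool := !s.isEmpty && s.all isdigit
def strIsalpha (s : _root_.List Char) : Bool := !s.isEmpty && s.all isalpha
def strIsalnum (s : _root_.List Char) : Bool := !s.isEmpty && s.all isalnum
def strIsspace (s : _root_.List Char) : Bool := !s.isEmpty && s.all isspace
def lower (s : _root_.List Char) : _root_.List Char := s.map lowerChar
def upper (s : _root_.List Char) : _root_.List Char := s.map upperChar

/-- `s.strip()` / `lstrip()` / `rstrip()` with no argument: Python's whitespace set. -/
def lstrip (s : _root_.List Char) : _root_.List Char := s.dropWhile isspace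
def rstrip (s : _root_.List Char) : _root_.List Char := (s.reverse.dropWhile isspace).reverse
def strip (s : _root_.List Char) : _root_.List Char := rstrip (lstrip s)
/-- `s.strip(chars)`: strip any of the given characters. -/
def stripChars (s chars : _root_.List Char) : _root_.List Char :=
  let p := fun c => chars.contains c
  ((s.dropWhile p).reverse.dropWhile p).reverse

/-- `s.split()` (no separator): split on RUNS of whitespace, no empty pieces. -/
def split₀ (s : _root_.List Char) : _root_.List (_root_.List Char) :=
  let rec go : _root_.List Char → _root_.List Char → _root_.List (_root_.List Char) → _root_.List (_root_.List Char)
    | [], cur, acc => if cur.isEmpty then acc.reverse else (cur.reverse :: acc).reverse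
    | c :: rest, cur, acc =>
      if isspace c then (if cur.isEmpty then go rest [] acc else go rest [] (cur.reverse :: acc))
      else go rest (c :: cur) acc
  go s [] []

/-- `s.split(sep)` for a NON-EMPTY separator: pieces left to right, empty pieces kept ('a,,b' → ['a','','b']). -/
def splitOn (s sep : _root_.List Char) : _root_.List (_root_.List Char) :=
  -- fuel = remaining length + 1 bounds the scan (each step consumes ≥ 1 character)
  let rec go : Nat → _root_.List Char → _root_.List Char → _root_.List (_root_.List Char) → _root_.List (_root_.List Char)
    | 0, l, cur, acc => ((cur.reverse ++ l) :: acc).reverse  -- out of fuel (only with an empty sep, which split? refuses): keep the rest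
    | _, [], cur, acc => (cur.reverse :: acc).reverse
    | fuel + 1, l@(c :: rest), cur, acc =>
      if sep.isPrefixOf l then go fuel (l.drop sep.length) [] (cur.reverse :: acc) else go fuel rest (c :: cur) acc
  go (s.length + 1) s [] []
/-- `s.split(sep)`: `none` = ValueError (empty separator). -/
def split? (s sep : _root_.List Char) : Option (_root_.List (_root_.List Char)) :=
  if sep.isEmpty then none else some (splitOn s sep)

/-- `s.splitlines()` (keepends=False): boundaries \n, \r\n, \r, \x0b, \x0c, \x1c, \x1d, \x1e, \x85, U+2028, U+2029; a trailing
boundary does not produce an empty last piece. -/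
def splitlines (s : _root_.List Char) : _root_.List (_root_.List Char) :=
  let isB := fun (c : Char) =>
    let n := c.toNat
    n = 10 || n = 13 || n = 11 || n = 12 || n = 28 || n = 29 || n = 30 || n = 0x85 || n = 0x2028 || n = 0x2029
  let rec go : _root_.List Char → _root_.List Char → _root_.List (_root_.List Char) → _root_.List (_root_.List Char)
    | [], cur, acc => if cur.isEmpty then acc.reverse else (cur.reverse :: acc).reverse
    | '\r' :: '\n' :: rest, cur, acc => go rest [] (cur.reverse :: acc)
    | c :: rest, cur, acc => if isB c then go rest [] (cur.reverse :: acc) else go rest (c :: cur) acc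
  go s [] []

/-- `sep.join(parts)`. -/
def join (sep : _root_.List Char) (parts : _root_.List (_root_.List Char)) : _root_.List Char := sep.intercalate parts

@[simp] theorem join_nil (sep : _root_.List Char) : join sep [] = [] := rfl
@[simp] theorem join_singleton (sep p : _root_.List Char) : join sep [p] = p := by simp [join, _root_.List.intercalate, _root_.List.intersperse]
theorem join_cons_cons (sep p q : _root_.List Char) (rest : _root_.List (_root_.List Char)) : join sep (p :: q :: rest) = p ++ sep ++ join sep (q :: rest) := by
  simp [join, _root_.List.intercalate]
/-- `''.join(map(str, cs))` of single characters is the string of those characters. -/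
@[simp] theorem join_nil_singletons (cs : _root_.List Char) : join [] (cs.map fun c => [c]) = cs := by
  induction cs with
  | nil => rfl
  | cons c t ih =>
    cases t with
    | nil => simp [join, _root_.List.intercalate]
    | cons d u => rw [_root_.List.map_cons, _root_.List.map_cons, join_cons_cons]; simpa using ih

/-- `s.startswith(p)` / `s.endswith(p)`. -/
def startswith (s p : _root_.List Char) : Bool := p.isPrefixOf s
def endswith (s p : _root_.List Char) : Bool := p.isSuffixOf s
/-- `s.find(sub)`: first code-point index or -1; `''` is found at 0. -/
def find (s sub : _root_.List Char) : _root_.Int :=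
  let rec go : _root_.List Char → Nat → _root_.Int
    | [], k => if sub.isEmpty then (k : _root_.Int) else -1
    | l@(_ :: t), k => if sub.isPrefixOf l then (k : _root_.Int) else go t (k + 1)
  go s 0
/-- `sub in s` (substring test; '' is in every string). -/
def isIn (sub s : _root_.List Char) : Bool := find s sub != -1
/-- `s.count(sub)`: non-overlapping occurrences; `s.count('')` = len(s)+1. -/
def count (s sub : _root_.List Char) : Nat :=
  if sub.isEmpty then s.length + 1 else
  let rec go : Nat → _root_.List Char → Nat → Nat
    | 0, _, acc => acc
    | _, [], acc => acc
    | fuel + 1, l@(_ :: t), acc => if sub.isPrefixOf l then go fuel (l.drop sub.length) (acc + 1) else go fuel t acc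
  go s.length s 0
/-- `s.replace(old, new)` (all occurrences, non-overlapping, left to right); `old = ''` inserts new before every character and at the end. -/
def replace (s old new : _root_.List Char) : _root_.List Char :=
  if old.isEmpty then new ++ (s.flatMap fun c => c :: new) else
  let rec go : Nat → _root_.List Char → _root_.List Char → _root_.List Char
    | 0, l, acc => acc.reverse ++ l
    | _, [], acc => acc.reverse
    | fuel + 1, l@(c :: t), acc => if old.isPrefixOf l then go fuel (l.drop old.length) (new.reverse ++ acc) else go fuel t (c :: acc)
  go s.length s []

/-- Python `len(s)` (code points). -/
def len (s : _root_.List Char) : _root_.Int := s.length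
/-- `s[i]` on code points, negative i from the end; `none` = IndexError. -/
def pyGet? (s : _root_.List Char) (i : _root_.Int) : Option Char := PySem.List.pyGet? s i
def slice (s : _root_.List Char) (start? stop? : Option _root_.Int := none) : _root_.List Char := PySem.List.slice s start? stop?
def slice? (s : _root_.List Char) (start? stop? : Option _root_.Int := none) (step : _root_.Int := 1) : Option (_root_.List Char) :=
  PySem.List.slice? s start? stop? step


-- ---- lemma pack 3: the Chars indexing/slicing wrappers ARE the List ones (simp moves to PySem.List, where the lemmas live); startswith as a prefix
@[simp] theorem pyGet?_eq_listPyGet? (s : _root_.List Char) (i : _root_.Int) : pyGet? s i = PySem.List.pyGet? s i := rfl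
@[simp] theorem slice_eq_listSlice (s : _root_.List Char) (a? b? : Option _root_.Int) : slice s a? b? = PySem.List.slice s a? b? := rfl
@[simp] theorem slice?_eq_listSlice? (s : _root_.List Char) (a? b? : Option _root_.Int) (st : _root_.Int) : slice? s a? b? st = PySem.List.slice? s a? b? st := rfl
@[simp] theorem len_eq (s : _root_.List Char) : len s = s.length := rfl
theorem startswith_iff (s p : _root_.List Char) : startswith s p = true ↔ p <+: s := by simp [startswith, _root_.List.isPrefixOf_iff_prefix]
theorem endswith_iff (s p : _root_.List Char) : endswith s p = true ↔ p <:+ s := by simp [endswith, _root_.List.isSuffixOf_iff_suffix]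

/-- Python `s.zfill(width)`: pad on the left with '0' up to `width` characters; a leading '+'/'-' sign stays in front of the
padding; a string already at least `width` long (or a non-positive width) is returned unchanged. Exact, no cap. -/
def zfill (cs : _root_.List Char) (w : _root_.Int) : _root_.List Char :=
  if w ≤ (cs.length : _root_.Int) then cs
  else
    match cs with
    | c :: rest =>
      if c = '+' ∨ c = '-' then c :: (_root_.List.replicate (w.toNat - cs.length) '0' ++ rest)
      else _root_.List.replicate (w.toNat - cs.length) '0' ++ cs
    | [] => _root_.List.replicate w.toNat '0'

theorem length_zfill (cs : _root_.List Char) (w : _root_.Int) : (zfill cs w).length = max cs.length w.toNat := by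
  unfold zfill
  by_cases hw : w ≤ (cs.length : _root_.Int)
  · rw [if_pos hw]; omega
  · rw [if_neg hw]
    cases cs with
    | nil => simp only [_root_.List.length_replicate, _root_.List.length_nil] at *; omega
    | cons c rest =>
      by_cases hc : c = '+' ∨ c = '-'
      · simp only [if_pos hc, _root_.List.length_cons, _root_.List.length_append, _root_.List.length_replicate] at *; omega
      · simp only [if_neg hc, _root_.List.length_cons, _root_.List.length_append, _root_.List.length_replicate] at *; omega


/-! ### Lemma pack 4 — str.find / 'sub in s' as a List infix, and where find points -/
private theorem find_go_spec (sub : _root_.List Char) : ∀ (l : _root_.List Char) (k : Nat),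
    (find.go sub l k ≠ -1 ↔ sub <:+: l) ∧ -1 ≤ find.go sub l k ∧ find.go sub l k ≤ k + l.length
  | [], k => by
    rw [find.go]
    cases sub with
    | nil => simp
    | cons c cs => simp
  | c :: t, k => by
    rw [find.go]
    split
    · rename_i hp
      have hp' : sub <+: c :: t := _root_.List.isPrefixOf_iff_prefix.mp hp
      refine ⟨⟨fun _ => hp'.isInfix, fun _ => by omega⟩, by omega, by simp; omega⟩
    · rename_i hp
      have hp' : ¬ sub <+: c :: t := fun h => hp (_root_.List.isPrefixOf_iff_prefix.mpr h)
      obtain ⟨h1, h2, h3⟩ := find_go_spec sub t (k + 1)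
      refine ⟨h1.trans ?_, h2, by simp; omega⟩
      rw [_root_.List.infix_cons_iff]; exact ⟨Or.inr, fun h => h.resolve_left hp'⟩
private theorem find_go_pos (sub : _root_.List Char) : ∀ (l : _root_.List Char) (k : Nat) (r : _root_.Int),
    find.go sub l k = r → 0 ≤ r → ∃ j : Nat, r = k + j ∧ sub <+: l.drop j ∧ ∀ i < j, ¬ sub <+: l.drop i
  | [], k, r, hr, h0 => by
    rw [find.go] at hr
    split at hr
    · rename_i he; subst hr
      have : sub = [] := by simpa using he
      exact ⟨0, by simp, by simp [this], by omega⟩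
    · omega
  | c :: t, k, r, hr, h0 => by
    rw [find.go] at hr
    split at hr
    · rename_i hp; subst hr
      exact ⟨0, by simp, by simpa using _root_.List.isPrefixOf_iff_prefix.mp hp, by omega⟩
    · rename_i hp
      obtain ⟨j, hj, hs, hm⟩ := find_go_pos sub t (k + 1) r hr h0
      refine ⟨j + 1, by omega, by simpa using hs, ?_⟩
      intro i hi
      cases i with
      | zero => simpa using fun h => hp (_root_.List.isPrefixOf_iff_prefix.mpr h)
      | succ i => simpa using hm i (by omega)
private theorem find_eq_go (s sub : _root_.List Char) : find s sub = find.go sub s 0 := rfl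
/-- s.find(sub) != -1  /  sub in s  is: sub occurs contiguously in s (List infix '<:+:'). -/
theorem find_ne_neg_one_iff (s sub : _root_.List Char) : find s sub ≠ -1 ↔ sub <:+: s := (find_go_spec sub s 0).1
theorem find_eq_neg_one_iff (s sub : _root_.List Char) : find s sub = -1 ↔ ¬ sub <:+: s := by
  rw [← find_ne_neg_one_iff]; exact Classical.not_not.symm
theorem neg_one_le_find (s sub : _root_.List Char) : -1 ≤ find s sub := (find_go_spec sub s 0).2.1
theorem find_le_length (s sub : _root_.List Char) : find s sub ≤ s.length := by have := (find_go_spec sub s 0).2.2; simpa using this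
theorem find_nonneg_iff (s sub : _root_.List Char) : 0 ≤ find s sub ↔ sub <:+: s := by
  rw [← find_ne_neg_one_iff]; have := neg_one_le_find s sub; omega
theorem isIn_iff_infix (sub s : _root_.List Char) : isIn sub s = true ↔ sub <:+: s := by
  rw [← find_ne_neg_one_iff]; simp [isIn, bne_iff_ne]
theorem isIn_eq_false_iff (sub s : _root_.List Char) : isIn sub s = false ↔ ¬ sub <:+: s := by
  rw [← isIn_iff_infix]; simp
@[simp] theorem isIn_nil (s : _root_.List Char) : isIn [] s = true := (isIn_iff_infix [] s).mpr _root_.List.nil_infix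
@[simp] theorem find_nil (s : _root_.List Char) : find s [] = 0 := by
  have h1 := (find_nonneg_iff s []).mpr _root_.List.nil_infix
  obtain ⟨j, hj, -, hm⟩ := find_go_pos [] s 0 _ rfl h1
  cases j with
  | zero => simpa [find_eq_go] using hj
  | succ j => exact absurd (_root_.List.nil_prefix) (hm 0 (by omega))
/-- WHERE s.find(sub) points when it is ≥ 0: sub starts there, and at no earlier position. -/
theorem find_spec {s sub : _root_.List Char} (h : 0 ≤ find s sub) :
    sub <+: s.drop (find s sub).toNat ∧ ∀ i < (find s sub).toNat, ¬ sub <+: s.drop i := by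
  obtain ⟨j, hj, hs, hm⟩ := find_go_pos sub s 0 _ rfl h
  rw [find_eq_go, hj]; simpa using ⟨hs, hm⟩
/-- 'some suffix of s starts with sub' (the form an index loop over s proves) is  sub in s. -/
theorem exists_prefix_drop_iff_isIn (sub s : _root_.List Char) : (∃ j : Nat, sub <+: s.drop j) ↔ isIn sub s = true := by
  rw [isIn_iff_infix]
  constructor
  · rintro ⟨j, hj⟩; exact hj.isInfix.trans (_root_.List.drop_suffix j s).isInfix
  · intro h; have h0 := (find_nonneg_iff s sub).mpr h; exact ⟨_, (find_spec h0).1⟩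

/-! ### Pack 5 — str.find with bounds, str.split with maxsplit. -/
/-- Python 's.find(sub, start, end)' (end omitted = none): start/end are read as SLICE bounds (negative from the end, end clamped to len),
the search runs inside s[start:end] and the answer is an index into s, or -1. CPython's one asymmetry is kept: a start beyond len(s) gives -1
even for the empty sub ('abc'.find('', 4) == -1 but 'abc'.find('', 3) == 3). -/
def findFrom (s sub : _root_.List Char) (start : _root_.Int) (end? : Option _root_.Int := none) : _root_.Int :=
  let n : _root_.Int := s.length
  let e : _root_.Int := match end? with
    | none => n
    | some e => if n < e then n else if e < 0 then (if e + n < 0 then 0 else e + n) else e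
  let st : _root_.Int := if start < 0 then (if start + n < 0 then 0 else start + n) else start
  if e < st then -1 else
    let r := find ((s.take e.toNat).drop st.toNat) sub
    if r = -1 then -1 else st + r
/-- Python 's.split(sep, maxsplit)' for a NON-EMPTY sep: at most maxsplit cuts (the rest stays in the last piece); maxsplit < 0 = no limit. -/
def splitOnMax (s sep : _root_.List Char) (maxsplit : _root_.Int) : _root_.List (_root_.List Char) :=
  if maxsplit < 0 then splitOn s sep else
  let rec go : Nat → Nat → _root_.List Char → _root_.List Char → _root_.List (_root_.List Char) → _root_.List (_root_.List Char)
    | 0, _, l, cur, acc => ((cur.reverse ++ l) :: acc).reverse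
    | _, _, [], cur, acc => (cur.reverse :: acc).reverse
    | fuel + 1, m, l@(c :: rest), cur, acc =>
      if m = 0 then ((cur.reverse ++ l) :: acc).reverse
      else if sep.isPrefixOf l then go fuel (m - 1) (l.drop sep.length) [] (cur.reverse :: acc) else go fuel m rest (c :: cur) acc
  go (s.length + 1) maxsplit.toNat s [] []
/-- Python 's.split(sep, maxsplit)': none = ValueError (empty sep). -/
def splitMax? (s sep : _root_.List Char) (maxsplit : _root_.Int) : Option (_root_.List (_root_.List Char)) :=
  if sep.isEmpty then none else some (splitOnMax s sep maxsplit)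
/-- Python 's.split(None, maxsplit)' / 's.split(maxsplit=n)': whitespace runs, at most maxsplit words split off, the remainder (leading
whitespace removed, trailing kept) as the last piece; maxsplit < 0 = s.split(). -/
def split₀Max (s : _root_.List Char) (maxsplit : _root_.Int) : _root_.List (_root_.List Char) :=
  if maxsplit < 0 then split₀ s else
  let rec go : Nat → Nat → _root_.List Char → _root_.List (_root_.List Char) → _root_.List (_root_.List Char)
    | 0, _, _, acc => acc.reverse
    | fuel + 1, m, l, acc =>
      match l.dropWhile isspace with
      | [] => acc.reverse
      | l' => if m = 0 then (l' :: acc).reverse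
              else go fuel (m - 1) (l'.dropWhile (fun c => !isspace c)) (l'.takeWhile (fun c => !isspace c) :: acc)
  go (s.length + 1) maxsplit.toNat s []

/-- Python 's.rfind(sub)': the HIGHEST index where sub starts, or -1 ('' is found at len(s)). -/
def rfind (s sub : _root_.List Char) : _root_.Int :=
  let rec go : Nat → _root_.Int
    | 0 => if sub.isPrefixOf s then 0 else -1
    | j + 1 => if sub.isPrefixOf (s.drop (j + 1)) then ((j + 1 : Nat) : _root_.Int) else go j
  go s.length
/-- Python 's.rfind(sub, start, end)': bounds as for findFrom (slice semantics; start past len(s) gives -1). -/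
def rfindFrom (s sub : _root_.List Char) (start : _root_.Int) (end? : Option _root_.Int := none) : _root_.Int :=
  let n : _root_.Int := s.length
  let e : _root_.Int := match end? with
    | none => n
    | some e => if n < e then n else if e < 0 then (if e + n < 0 then 0 else e + n) else e
  let st : _root_.Int := if start < 0 then (if start + n < 0 then 0 else start + n) else start
  if e < st then -1 else
    let r := rfind ((s.take e.toNat).drop st.toNat) sub
    if r = -1 then -1 else st + r
/-- Python's  s < t  on str compares code points lexicographically — that IS Lean's '<' on List Char (and on String): port 's < t' as
's.toList < t.toList' (decidable; List.Lex lemmas apply). This Bool form is for ports that store the comparison. -/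
def strLt (s t : _root_.List Char) : Bool := decide (s < t)

/-- s.find(sub, k) from a natural start k ≤ len(s) is the plain find on s[k:], re-based (so find_ne_neg_one_iff / find_spec apply to it). -/
theorem findFrom_natCast (s sub : _root_.List Char) (k : Nat) (hk : k ≤ s.length) :
    findFrom s sub (k : _root_.Int) none = (if find (s.drop k) sub = -1 then -1 else (k : _root_.Int) + find (s.drop k) sub) := by
  unfold findFrom
  have h1 : ¬ ((k : _root_.Int) < 0) := by omega
  have h2 : ¬ ((s.length : _root_.Int) < (k : _root_.Int)) := by omega
  simp only [h1, h2, ↓reduceIte, Int.toNat_natCast, _root_.List.take_length]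
@[simp] theorem findFrom_zero (s sub : _root_.List Char) : findFrom s sub 0 none = find s sub := by
  rw [show (0 : _root_.Int) = ((0 : Nat) : _root_.Int) by rfl, findFrom_natCast s sub 0 (by omega)]
  simp only [_root_.List.drop_zero]; split <;> simp_all
theorem findFrom_natCast_eq_neg_one_iff (s sub : _root_.List Char) (k : Nat) (hk : k ≤ s.length) :
    findFrom s sub (k : _root_.Int) none = -1 ↔ ¬ sub <:+: s.drop k := by
  rw [findFrom_natCast s sub k hk, ← find_eq_neg_one_iff]
  have := neg_one_le_find (s.drop k) sub
  split <;> constructor <;> intro h <;> first | assumption | omega | simp_all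
/-- WHERE s.find(sub, k) points when it is not -1: at or after k, sub starts there, and nowhere in between. -/
theorem findFrom_natCast_spec (s sub : _root_.List Char) (k : Nat) (hk : k ≤ s.length) (h : findFrom s sub (k : _root_.Int) none ≠ -1) :
    (k : _root_.Int) ≤ findFrom s sub k none ∧ sub <+: s.drop (findFrom s sub k none).toNat ∧
      ∀ i : Nat, k ≤ i → i < (findFrom s sub k none).toNat → ¬ sub <+: s.drop i := by
  rw [findFrom_natCast s sub k hk] at h ⊢
  by_cases hf : find (s.drop k) sub = -1
  · simp [hf] at h
  · simp only [hf, ↓reduceIte]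
    have h0 : 0 ≤ find (s.drop k) sub := by have := neg_one_le_find (s.drop k) sub; omega
    obtain ⟨h1, h2⟩ := find_spec h0
    have e : ∀ j, (s.drop k).drop j = s.drop (k + j) := fun j => by simp [_root_.List.drop_drop]
    refine ⟨by omega, ?_, ?_⟩
    · rw [show ((k : _root_.Int) + find (s.drop k) sub).toNat = k + (find (s.drop k) sub).toNat by omega, ← e]; exact h1
    · intro i hki hi
      have := h2 (i - k) (by omega)
      rwa [e, show k + (i - k) = i by omega] at this
theorem splitMax?_of_neg (s sep : _root_.List Char) {m : _root_.Int} (h : m < 0) : splitMax? s sep m = split? s sep := by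
  simp [splitMax?, split?, splitOnMax, h]
theorem split₀Max_of_neg (s : _root_.List Char) {m : _root_.Int} (h : m < 0) : split₀Max s m = split₀ s := by
  simp [split₀Max, h]

end Chars

/-! `PySem.Str`: the same API on `String` — thin wrappers over `PySem.Chars`; `simp` with the bridge lemma moves a goal to the list form. -/
namespace Str

def isspace := Chars.isspace
def isdigit := Chars.isdigit
def isalpha := Chars.isalpha
def isalnum := Chars.isalnum
def isupper := Chars.isupper
def islower := Chars.islower
def strIsdigit (s : String) : Bool := Chars.strIsdigit s.toList
def strIsalpha (s : String) : Bool := Chars.strIsalpha s.toList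
def strIsalnum (s : String) : Bool := Chars.strIsalnum s.toList
def strIsspace (s : String) : Bool := Chars.strIsspace s.toList
def lower (s : String) : String := String.ofList (Chars.lower s.toList)
def upper (s : String) : String := String.ofList (Chars.upper s.toList)
def lstrip (s : String) : String := String.ofList (Chars.lstrip s.toList)
def rstrip (s : String) : String := String.ofList (Chars.rstrip s.toList)
def strip (s : String) : String := String.ofList (Chars.strip s.toList)
def stripChars (s chars : String) : String := String.ofList (Chars.stripChars s.toList chars.toList)
def split₀ (s : String) : _root_.List String := (Chars.split₀ s.toList).map String.ofList
def split? (s sep : String) : Option (_root_.List String) := (Chars.split? s.toList sep.toList).map (·.map String.ofList)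
def splitlines (s : String) : _root_.List String := (Chars.splitlines s.toList).map String.ofList
def join (sep : String) (parts : _root_.List String) : String := String.ofList (Chars.join sep.toList (parts.map String.toList))
def startswith (s p : String) : Bool := Chars.startswith s.toList p.toList
def endswith (s p : String) : Bool := Chars.endswith s.toList p.toList
def find (s sub : String) : _root_.Int := Chars.find s.toList sub.toList
/-- `sub in s`. -/
def isIn (sub s : String) : Bool := Chars.isIn sub.toList s.toList
def count (s sub : String) : Nat := Chars.count s.toList sub.toList
def replace (s old new : String) : String := String.ofList (Chars.replace s.toList old.toList new.toList)
/-- Python `len(s)`: code points (= s.toList.length; Lean's own String.length is an opaque constant to the kernel). -/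
def len (s : String) : _root_.Int := s.toList.length
@[simp] theorem len_eq (s : String) : len s = s.toList.length := rfl
def pyGet? (s : String) (i : _root_.Int) : Option Char := Chars.pyGet? s.toList i
def slice (s : String) (start? stop? : Option _root_.Int := none) : String := String.ofList (Chars.slice s.toList start? stop?)
def slice? (s : String) (start? stop? : Option _root_.Int := none) (step : _root_.Int := 1) : Option String :=
  (Chars.slice? s.toList start? stop? step).map String.ofList

-- bridge lemmas: one 'simp' moves a String-level goal to the List Char definitions
@[simp] theorem toList_lower (s : String) : (lower s).toList = Chars.lower s.toList := by simp [lower]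

/-- Python `s.zfill(width)` (see Chars.zfill). -/
def zfill (s : String) (w : _root_.Int) : String := String.ofList (Chars.zfill s.toList w)

@[simp] theorem toList_zfill (s : String) (w : _root_.Int) : (zfill s w).toList = Chars.zfill s.toList w := by simp [zfill]
@[simp] theorem toList_upper (s : String) : (upper s).toList = Chars.upper s.toList := by simp [upper]
@[simp] theorem toList_strip (s : String) : (strip s).toList = Chars.strip s.toList := by simp [strip]
@[simp] theorem toList_lstrip (s : String) : (lstrip s).toList = Chars.lstrip s.toList := by simp [lstrip]
@[simp] theorem toList_rstrip (s : String) : (rstrip s).toList = Chars.rstrip s.toList := by simp [rstrip]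
@[simp] theorem toList_replace (s o n : String) : (replace s o n).toList = Chars.replace s.toList o.toList n.toList := by simp [replace]
@[simp] theorem toList_slice (s : String) (a? b? : Option _root_.Int) : (slice s a? b?).toList = Chars.slice s.toList a? b? := by simp [slice]
@[simp] theorem toList_join (sep : String) (parts : _root_.List String) :
    (join sep parts).toList = Chars.join sep.toList (parts.map String.toList) := by simp [join]
@[simp] theorem split₀_map_toList (s : String) : (split₀ s).map String.toList = Chars.split₀ s.toList := by simp [split₀, Function.comp_def]
@[simp] theorem splitlines_map_toList (s : String) : (splitlines s).map String.toList = Chars.splitlines s.toList := by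
  simp [splitlines, Function.comp_def]
@[simp] theorem strIsdigit_eq (s : String) : strIsdigit s = Chars.strIsdigit s.toList := rfl
@[simp] theorem strIsalpha_eq (s : String) : strIsalpha s = Chars.strIsalpha s.toList := rfl
@[simp] theorem strIsalnum_eq (s : String) : strIsalnum s = Chars.strIsalnum s.toList := rfl
@[simp] theorem strIsspace_eq (s : String) : strIsspace s = Chars.strIsspace s.toList := rfl
@[simp] theorem find_eq (s t : String) : find s t = Chars.find s.toList t.toList := rfl
@[simp] theorem isIn_eq (s t : String) : isIn s t = Chars.isIn s.toList t.toList := rfl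
@[simp] theorem count_eq (s t : String) : count s t = Chars.count s.toList t.toList := rfl
@[simp] theorem startswith_eq (s t : String) : startswith s t = Chars.startswith s.toList t.toList := rfl
@[simp] theorem endswith_eq (s t : String) : endswith s t = Chars.endswith s.toList t.toList := rfl
@[simp] theorem pyGet?_eq (s : String) (i : _root_.Int) : pyGet? s i = Chars.pyGet? s.toList i := rfl
@[simp] theorem toList_stripChars (s c : String) : (stripChars s c).toList = Chars.stripChars s.toList c.toList := by simp [stripChars]
@[simp] theorem split?_map (s sep : String) : (split? s sep).map (·.map String.toList) = Chars.split? s.toList sep.toList := by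
  simp [split?, Chars.split?]; split <;> simp [Function.comp_def]
@[simp] theorem slice?_map (s : String) (a? b? : Option _root_.Int) (st : _root_.Int) : (slice? s a? b? st).map String.toList = Chars.slice? s.toList a? b? st := by
  simp [slice?, Function.comp_def]


/-! ### Lemma pack 4 — Str-level corollaries -/
theorem isIn_iff_infix (sub s : String) : isIn sub s = true ↔ sub.toList <:+: s.toList := Chars.isIn_iff_infix _ _
theorem find_ne_neg_one_iff (s sub : String) : find s sub ≠ -1 ↔ sub.toList <:+: s.toList := Chars.find_ne_neg_one_iff _ _
theorem find_eq_neg_one_iff (s sub : String) : find s sub = -1 ↔ ¬ sub.toList <:+: s.toList := Chars.find_eq_neg_one_iff _ _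
theorem find_nonneg_iff (s sub : String) : 0 ≤ find s sub ↔ sub.toList <:+: s.toList := Chars.find_nonneg_iff _ _
/-- s[::-1] on a String. -/
theorem slice?_none_none_neg_one (s : String) : slice? s none none (-1) = some (String.ofList s.toList.reverse) := by
  simp [slice?, PySem.List.slice?_none_none_neg_one]
theorem slice_to_neg_one (s : String) : (slice s none (some (-1))).toList = s.toList.dropLast := by
  simp [PySem.List.slice_to_neg_one]
@[simp] theorem pyGet?_natCast (s : String) (n : Nat) : pyGet? s (n : _root_.Int) = s.toList[n]? := by simp

/-! ### Pack 5 — Str wrappers -/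
def findFrom (s sub : String) (start : _root_.Int) (end? : Option _root_.Int := none) : _root_.Int := Chars.findFrom s.toList sub.toList start end?
def splitMax? (s sep : String) (maxsplit : _root_.Int) : Option (_root_.List String) := (Chars.splitMax? s.toList sep.toList maxsplit).map (·.map String.ofList)
def split₀Max (s : String) (maxsplit : _root_.Int) : _root_.List String := (Chars.split₀Max s.toList maxsplit).map String.ofList
@[simp] theorem findFrom_eq (s sub : String) (st : _root_.Int) (e? : Option _root_.Int) : findFrom s sub st e? = Chars.findFrom s.toList sub.toList st e? := rfl
@[simp] theorem splitMax?_map (s sep : String) (m : _root_.Int) : (splitMax? s sep m).map (·.map String.toList) = Chars.splitMax? s.toList sep.toList m := by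
  simp [splitMax?, Chars.splitMax?]; split <;> simp [Function.comp_def]
@[simp] theorem split₀Max_map_toList (s : String) (m : _root_.Int) : (split₀Max s m).map String.toList = Chars.split₀Max s.toList m := by
  simp [split₀Max, Function.comp_def]
def rfind (s sub : String) : _root_.Int := Chars.rfind s.toList sub.toList
def rfindFrom (s sub : String) (start : _root_.Int) (end? : Option _root_.Int := none) : _root_.Int := Chars.rfindFrom s.toList sub.toList start end?
@[simp] theorem rfind_eq (s t : String) : rfind s t = Chars.rfind s.toList t.toList := rfl
@[simp] theorem rfindFrom_eq (s t : String) (st : _root_.Int) (e? : Option _root_.Int) : rfindFrom s t st e? = Chars.rfindFrom s.toList t.toList st e? := rfl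

-- ---- lemma pack 6: len against String.length, len of a concatenation
/-- len(s) against Lean's String.length (= code points too). -/
theorem len_eq_length (s : String) : len s = s.length := by simp [len]
theorem len_append (s t : String) : len (s ++ t) = len s + len t := by simp [len]

end Str

end PySem
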